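/- GENERATED by mk_final_copies.py from the proof of the farm's unit `start_decoder.C2` (farm:start_decoder.C2.2: Lemmas.lean) as the
   re-elaboration sweep compiled it — do not edit. -/
import Asan.CheckWalk
import Vorbis.Spec.StartDecoderATest
import Vorbis.Spec.StartDecoderBTest
import Vorbis.Spec.StartDecoderCarry
import Vorbis.Spec.ReaderLemmas
import Vorbis.Spec.Units.start_decoder_C2
open X86 X86.User Asan Vorbis Vorbis.Spec Vorbis.Spec.StartDecoder

set_option maxRecDepth 100000
set_option maxHeartbeats 4000000

namespace Vorbis.Spec.start_decoder_C2

/-- A stack slot of the steady frame, as the word the walker computes: `R + j = RA - (1480 - j)`. -/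
theorem slot_word (x : Word) (j : Nat) (hj : j ≤ 1480) (hx : 1480 ≤ x.toNat) :
    addr (x.toNat - 1480 + j) = x - UInt64.ofNat (1480 - j) := by
  symm
  apply eq_addr
  u_omega

/-- The return-address slot of a call from the steady frame: `R - 8 = RA - 1488`. -/
theorem sub_1488 (x : Word) : x - 1480 - 8 = x - 1488 := by
  apply UInt64.eq_of_toBitVec_eq
  simp only [UInt64.toBitVec_sub]
  generalize x.toBitVec = b
  bv_decide

/-- **Where `*f` is, relative to start_decoder's own stack** (one arithmetic fact for `u_omega`): `*f` lies inside ONE live object of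
the callers' frames (`Hand.obj`) — above the return-address slot (`Frame.callers`) — or of `A.2` — off the stack region
(`ShadowInv.off`). So no push, spill or callee frame of start_decoder meets it. -/
theorem f_where {u₀ : State} {g : Ghost} {pc : Word} {A : Arena × List Obj} {v : State}
    (hfr : Frame u₀ g pc A v) (hh : g.Hand A) :
    0x119d40 ≤ g.f ∧ g.f + 1808 ≤ 0xC00000 ∧ (g.RA + 8 ≤ g.f ∨ g.f + 1808 ≤ 0x700000 ∨ 0x800000 ≤ g.f) := by
  have hl : LiveIn A.2 g.frames' g.f Off.sizeof.stb_vorbis := hh.obj.mono (sub_frames' g A)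
  have hw := hl.where_ hfr.shadow hfr.offText (by decide)
  simp only [Off.sizeof.stb_vorbis] at hw
  refine ⟨hw.1, hw.2.1, ?_⟩
  obtain ⟨o, ho, h1, h2⟩ := hh.obj
  simp only [Off.sizeof.stb_vorbis] at h2
  rcases List.mem_append.mp ho with hs | hoth
  · -- an object of a caller's protected frame
    unfold stackObjs at hs
    obtain ⟨bF, hbF, hin⟩ := List.mem_flatMap.mp hs
    have hmem : bF ∈ g.frames' := List.mem_cons_of_mem _ hbF
    obtain ⟨k1, k2, _, _, _⟩ := hfr.shadow.stack.active bF hmem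
    have hg := FrameLayout.objsAt_gran k1 k2 hin
    have hc := hfr.callers bF hbF
    have hra := hfr.ra.1
    have e : o.gLo = o.base / 8 := rfl
    left
    omega
  · have := hfr.shadow.off o hoth
    unfold OffStack at this
    omega

/-- **The windows of `*f` that `SDw len 3` reads BESIDES the arena's four fields and the bit reader's** (S5's `Mid.winsAt` for the
first half): `sample_rate`, `channels`; `blocksize_0` … `codebooks` and the zero rest up to the paging fields; `first_decode`;
`discard_samples_deferred`. A reader call, `error` (`[140, 144)`), an allocator call (`[8, 12)`, `[128, 136)`) write none of them. -/
def sdwWins : Wins := [(0, 8), (152, 1480), (1749, 1750), (1784, 1788)]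

/-- **FRAME OF `SDw len 3`** (the missing analogue of S5's `Mid.frame`): over a callee or a batch of stores that leaves the windows
`sdwWins` of `*f`, the frame constants `[R + 8, R + 28H)` and the shadow alone; the arena layer and `Bits` are given for the new
memory (`ArenaOK.frame`; the reader's post / `Bits.frame_fields`). No block content is read by `SDw 3`. -/
theorem sdw_frame {len : Nat} {A : Arena × List Obj} {Blk : Block → Prop} {Live : Nat → Prop} {mem mem' : Mem} {f R : Nat}
    (h : SDw len 3 A Blk Live mem f R) (he : ObjEq sdwWins mem f mem' f)
    (hconsts : Mem.EqOn (R + 8) (R + 0x28) mem mem') (hR : R + 0x28 ≤ 2 ^ 64)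
    (hsh : Mem.EqOn 0xC00000 0xE00000 mem mem') (harena : ArenaOK A.1 A.2 mem' f) (hbits : Bits Blk len mem' f) :
    SDw len 3 A Blk Live mem' f R := by
  have m0 : ((0, 8) : Nat × Nat) ∈ sdwWins := List.mem_cons_self
  have m1 : ((152, 1480) : Nat × Nat) ∈ sdwWins := List.mem_cons_of_mem _ List.mem_cons_self
  refine ⟨h.env.eqOn hsh, h.frame.frame hconsts hR, harena, h.setups, hbits, ?_, ?_, ?_, ?_, ?_⟩
  · have e : stb_vorbis.first_decode mem' f = stb_vorbis.first_decode mem f := by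
      simp only [vacc, voff]
      exact he.u8 1749 (by decide)
    rw [e]
    exact h.first
  · have e : stb_vorbis.discard_samples_deferred mem' f = stb_vorbis.discard_samples_deferred mem f := by
      simp only [vacc, voff]
      exact he.i32 1784 (by decide)
    rw [e]
    exact h.discard0
  · intro h1
    apply (h.header h1).transfer
    exact he.sub (by decide)
  · intro h3
    obtain ⟨hc, hne⟩ := h.cb0 h3
    refine ⟨hc.transfer (he.sub (by decide)) (fun _ _ hb => hb), ?_⟩
    have e : stb_vorbis.codebooks mem' f = stb_vorbis.codebooks mem f := by
      simp only [vacc, voff]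
      exact he.u64 168 (by decide)
    rw [e]
    exact hne
  · intro o ho1 ho2
    have hz := h.rest o ho1 ho2
    have hlo : 176 ≤ o := by
      have : restFrom 3 = 176 := by decide
      omega
    simp only [voff] at ho2
    rw [he (152, 1480) m1 o (by omega) ho2]
    exact hz

/-- **What segment C2 carries from its entry to every exit** (the memory-dependent clauses of `BodyC2` / `Cur` that the code in
between does not establish itself): SD.3 in its weak form, the record with the ages, ZF(i), the two spill slots. `A2 A3` are the
ghost snapshots of `BodyC2.ages`; the head-of-iteration snapshot is the arena `A.1` of the entry. -/
structure Carry (g : Ghost) (i : Nat) (A2 A3 : Arena) (A : Arena × List Obj) (mem : Mem) : Prop where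
  sdw : SDw g.len 3 A (g.Blk A) (g.Live A) mem g.f g.R
  ages : BookTrans A2 A3 A.1 A.1 mem g.f i
  zf : ZF mem (stb_vorbis.codebooks mem g.f) (stb_vorbis.codebook_count mem g.f).toNat i
  slot_f : mem.u64 (g.R + 0x18) = g.f
  slot_i : mem.u32 (g.R + 0x30) = i

/-- The entry assertion of C2 gives the carried clauses. -/
theorem Carry.of_body {u₀ : State} {g : Ghost} {i : Nat} {A : Arena × List Obj} {v : State} (hb : BodyC2 u₀ g i A v) :
    ∃ A2 A3, Carry g i A2 A3 A v.mem := by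
  obtain ⟨A2, A3, ha⟩ := hb.ages
  exact ⟨A2, A3, Cur.sd_of_sd4 hb.sd, ha, hb.sd.zf, hb.slot_f, hb.slot_i⟩

/-- The windows of `*f` the carried clauses read besides the arena's and the reader's fields: `sdwWins` + `BookTrans.wins`. -/
def carryWins : Wins := [(0, 8), (24, 48), (152, 1480), (1749, 1750), (1784, 1788)]

/-- **FRAME of the carried clauses** over a callee / a batch of stores that keeps every setup block of the arena (a reader, `error`, an
allocator, a push: they write `*f`, the stack and shadow bytes only), leaves the windows `carryWins` of `*f`, the frame slots
`[R + 8, R + 38H)` and the shadow alone. -/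
theorem Carry.frame {g : Ghost} {i : Nat} {A2 A3 : Arena} {A : Arena × List Obj} {mem mem' : Mem}
    (h : Carry g i A2 A3 A mem) (he : ObjEq carryWins mem g.f mem' g.f) (hk : AllKept A.1.Blk mem mem')
    (hslots : Mem.EqOn (g.R + 8) (g.R + 0x38) mem mem') (hR : g.R + 0x38 ≤ 2 ^ 64)
    (hsh : Mem.EqOn 0xC00000 0xE00000 mem mem') (harena : ArenaOK A.1 A.2 mem' g.f)
    (hbits : Bits (g.Blk A) g.len mem' g.f) : Carry g i A2 A3 A mem' := by
  have ecnt : stb_vorbis.codebook_count mem' g.f = stb_vorbis.codebook_count mem g.f := by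
    simp only [vacc, voff]
    exact he.i32 160 (by decide)
  have ecbs : stb_vorbis.codebooks mem' g.f = stb_vorbis.codebooks mem g.f := by
    simp only [vacc, voff]
    exact he.u64 168 (by decide)
  have hages := h.ages.frame_old (he.sub (by decide)) hk
  refine ⟨sdw_frame h.sdw (he.sub (by decide)) (hslots.mono (Nat.le_refl _) (by omega)) (by omega) hsh harena hbits,
    hages, ?_, ?_, ?_⟩
  · -- ZF(i): the codebooks block is kept
    rw [ecnt, ecbs]
    have hF1 := h.ages.F1
    have hle := h.ages.n_le
    have hkept := hk _ h.ages.cbOK.F2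
    apply h.zf.same
    · apply Mem.EqOn.mono hkept.same
      · simp only []
        exact Nat.le_add_right _ _
      · exact Nat.le_refl _
    · omega
    · exact hkept.inside
  · rw [hslots.u64 (g.R + 0x18) (by omega) (by omega) hR]
    exact h.slot_f
  · rw [hslots.u32 (g.R + 0x30) (by omega) (by omega) hR]
    exact h.slot_i

/-- FRAME of SH7 for `log2_4`: the sixteen bytes of the table read the same. -/
theorem log2_frame {mem mem' : Mem} (h : Log2_4In mem) (he : Mem.EqOn 0x120640 0x120650 mem mem') : Log2_4In mem' := by
  intro j hj
  rw [← h j hj]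
  have e : (UInt64.ofNat (Vorbis.Globals.log2_4.beg + j)).toNat = 0x120640 + j := by
    have : Vorbis.Globals.log2_4.beg = 0x120640 := rfl
    rw [this, UInt64.toNat_ofNat']
    omega
  exact he.readLE _ 1 (by omega) (by omega) (by omega)

/-- **A window of a footprint that the carried clauses tolerate without further ado**: inside start_decoder's stack below the steady
stack pointer (a pushed return address, a callee's frame), or inside one of the fields of `*f` that the readers and `error`
write (`stream`, the page fields, `eof`, `error`, the segment table … `valid_bits`). -/
def OKSpan (g : Ghost) (s : Span) : Prop :=
  (g.RA - depth ≤ s.lo ∧ s.hi ≤ g.R) ∨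
    (g.f + 48 ≤ s.lo ∧ s.hi ≤ g.f + 56) ∨ (g.f + 84 ≤ s.lo ∧ s.hi ≤ g.f + 96) ∨ (g.f + 136 ≤ s.lo ∧ s.hi ≤ g.f + 144) ∨
    (g.f + 1484 ≤ s.lo ∧ s.hi ≤ g.f + 1749) ∨ (g.f + 1752 ≤ s.lo ∧ s.hi ≤ g.f + 1784)

/-- **ONE STEP OF SEGMENT C2 THAT ALLOCATES NOTHING AND STORES INTO NO ARENA BLOCK** (a check call, a `get_bits`, an `error`): the
common part `Frame` at the new program counter and the carried clauses, from the machine-level facts of the new state `w` — its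
footprint `hs` relative to the cut-point state `v`, every window an `OKSpan` — and `Bits` of the new memory (the reader's post,
or `store_off_obj`). -/
theorem stepC {u₀ : State} {g : Ghost} {pc pc' : Word} {i : Nat} {A2 A3 : Arena} {A : Arena × List Obj} {v w : State}
    (hfr : Frame u₀ g pc A v) (hh : g.Hand A) (hc : Carry g i A2 A3 A v.mem) {ws : List Span}
    (hs : Mem.SameExcept ws v.mem w.mem) (hws : ∀ s, s ∈ ws → OKSpan g s)
    (hrip : w.rip = pc') (hrsp : w.reg .rsp = addr g.R) (hcode : CodeOK u₀ w.mem) (hinv : abiInv w)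
    (hbits : Bits (g.Blk A) g.len w.mem g.f) :
    Frame u₀ g pc' A w ∧ Carry g i A2 A3 A w.mem ∧ ObjEq carryWins v.mem g.f w.mem g.f ∧ AllKept A.1.Blk v.mem w.mem := by
  obtain ⟨hw1, hw2, hw3⟩ := f_where hfr hh
  obtain ⟨hr1, hr2⟩ := hfr.r_eq
  obtain ⟨ha1, ha2, ha3⟩ := hfr.ra
  simp only [depth, steady] at hr1 ha2
  have harena := hc.sdw.arena
  have hAR1 := harena.AR1
  have hout := hh.objOut
  simp only [voff] at hout
  -- every window, as arithmetic: off the shadow, off the frame slots, off the arena, off the windows of `*f` that are read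
  have hspan : ∀ s, s ∈ ws → s.hi ≤ 0xC00000 ∧
      ((g.RA - 1888 ≤ s.lo ∧ s.hi ≤ g.R) ∨
        (g.f + 48 ≤ s.lo ∧ s.hi ≤ g.f + 56) ∨ (g.f + 84 ≤ s.lo ∧ s.hi ≤ g.f + 96) ∨ (g.f + 136 ≤ s.lo ∧ s.hi ≤ g.f + 144) ∨
        (g.f + 1484 ≤ s.lo ∧ s.hi ≤ g.f + 1749) ∨ (g.f + 1752 ≤ s.lo ∧ s.hi ≤ g.f + 1784)) := by
    intro s hsm
    have := hws s hsm
    unfold OKSpan at this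
    simp only [depth] at this
    refine ⟨?_, this⟩
    omega
  have hun : Mem.EqOn 0xC00000 0xE00000 v.mem w.mem := by
    apply hs.eqOn
    intro s hsm
    have := (hspan s hsm).1
    omega
  have hslots : Mem.EqOn (g.R + 8) (g.R + 0x38) v.mem w.mem := by
    apply hs.eqOn
    intro s hsm
    have := (hspan s hsm).2
    omega
  have hsaved : Mem.EqOn (g.R + 0x598) (g.R + 0x5d0) v.mem w.mem := by
    apply hs.eqOn
    intro s hsm
    have := (hspan s hsm).2
    omega
  have hflds : Mem.EqOn (g.f + 112) (g.f + 136) v.mem w.mem := by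
    apply hs.eqOn
    intro s hsm
    have := (hspan s hsm).2
    omega
  have hlog : Mem.EqOn 0x120640 0x120650 v.mem w.mem := by
    have hblk : g.Blk A (objBlock g.f) := runBlk_extra List.mem_cons_self
    have hblk2 : g.Blk A ⟨0x120640, 16⟩ := by
      apply runBlk_extra
      simp only [fixedBlocks, globalBlocks, List.mem_cons, true_or, or_true]
    have hd := hc.sdw.env.ok.disjoint hblk hblk2 (by
      intro e
      have := congrArg Block.size e
      simp only [vblock, voff] at this
      omega)
    simp only [vblock, voff] at hd
    apply hs.eqOn
    intro s hsm
    have := (hspan s hsm).2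
    omega
  have hobj : ObjEq carryWins v.mem g.f w.mem g.f := by
    apply ObjEq.of_sameExcept hs
    · intro win hwin
      simp only [carryWins, List.mem_cons, List.mem_nil_iff, or_false] at hwin
      rcases hwin with rfl | rfl | rfl | rfl | rfl <;> simp only [] <;> omega
    · intro win hwin s hsm
      have := (hspan s hsm).2
      simp only [carryWins, List.mem_cons, List.mem_nil_iff, or_false] at hwin
      rcases hwin with rfl | rfl | rfl | rfl | rfl <;> simp only [] <;> omega
  have hkept : AllKept A.1.Blk v.mem w.mem := by
    apply AllKept.of_sameExcept harena.blkOK hs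
    intro B hB s hsm
    have := (hspan s hsm).2
    have hin := arena_inside harena hB
    have hoff := harena.blk_off_stack hB
    omega
  have harena' : ArenaOK A.1 A.2 w.mem g.f := by
    apply harena.frame (by simp only [voff]; omega)
    simp only [voff]
    exact hflds
  have hR64 : g.R + 0x5d0 ≤ 2 ^ 64 := by omega
  refine ⟨?_, hc.frame hobj hkept hslots (by omega) hun harena' hbits, hobj, hkept⟩
  exact
    { entry := hfr.entry
      rip := hrip
      rsp := hrsp
      shadowIdx := by
        rw [hslots.u64 (g.R + 8) (by omega) (by omega) (by omega)]
        exact hfr.shadowIdx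
      saved_rbx := by
        rw [hsaved.u64 (g.R + 0x598) (by omega) (by omega) hR64]
        exact hfr.saved_rbx
      saved_rbp := by
        rw [hsaved.u64 (g.R + 0x5a0) (by omega) (by omega) hR64]
        exact hfr.saved_rbp
      saved_r12 := by
        rw [hsaved.u64 (g.R + 0x5a8) (by omega) (by omega) hR64]
        exact hfr.saved_r12
      saved_r13 := by
        rw [hsaved.u64 (g.R + 0x5b0) (by omega) (by omega) hR64]
        exact hfr.saved_r13
      saved_r14 := by
        rw [hsaved.u64 (g.R + 0x5b8) (by omega) (by omega) hR64]
        exact hfr.saved_r14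
      saved_r15 := by
        rw [hsaved.u64 (g.R + 0x5c0) (by omega) (by omega) hR64]
        exact hfr.saved_r15
      saved_ra := by
        rw [hsaved.u64 (g.R + 0x5c8) (by omega) (by omega) hR64]
        exact hfr.saved_ra
      code := hcode
      inv := hinv
      shadow := hfr.shadow.untouched hun
      offText := hfr.offText
      ext := hfr.ext
      callers := hfr.callers
      sh7 := log2_frame hfr.sh7 hlog
      same := by
        apply hfr.same.step_same hs
        intro s hsm a h1 h2
        have := (hspan s hsm).2
        unfold footprint writes
        rcases this with hst | hfl
        · refine ⟨⟨g.RA - depth, g.RA⟩, List.mem_cons_self, ?_, ?_⟩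
          · simp only [depth]
            omega
          · simp only []
            omega
        · refine ⟨(objBlock (g.e.reg .rdi).toNat).span, List.mem_cons_of_mem _ List.mem_cons_self, ?_, ?_⟩
          · have e : (g.e.reg .rdi).toNat = g.f := rfl
            simp only [vblock, voff, e]
            omega
          · have e : (g.e.reg .rdi).toNat = g.f := rfl
            simp only [vblock, voff, e]
            omega }

/-- **Back to `SD4 i`** (the exits at a loop head: `AtC16`): the carried clauses and `temps = []` (memory-independent). -/
theorem Carry.sd4 {g : Ghost} {i : Nat} {A2 A3 : Arena} {A : Arena × List Obj} {mem : Mem}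
    (hc : Carry g i A2 A3 A mem) (hno : A.1.temps = []) :
    Real.SD4 g.len i A (g.Blk A) (g.Live A) mem g.f g.R := by
  have hown := hc.ages.upTo
  have hcm : CommentsOK (g.Blk A) mem g.f :=
    CommentsOK.reblk (hown.own.comment (by omega)) (fun B _ hB => up g A B hB)
  exact
    { toSD := hc.sdw.toSD (by omega) hno (fun h1 => absurd h1 (by omega)) (fun _ => hcm)
      done := ⟨(hc.sdw.cb0 (by omega)).1, (hc.sdw.cb0 (by omega)).2, hc.ages.n_le,
        fun j hj => CodebookOK.reblk (hown.books j hj) (fun B _ hB => up g A B hB)⟩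
      zf := hc.zf }

/-- **The exit `AtC16`** (0x1151bf, `count ≤ i`) from the common part at that address and the carried clauses. -/
theorem Carry.toC16 {u₀ : State} {g : Ghost} {i : Nat} {A2 A3 : Arena} {A : Arena × List Obj} {w : State}
    (hfr : Frame u₀ g pc_C16 A w) (hh : g.Hand A) (hc : Carry g i A2 A3 A w.mem) (hno : A.1.temps = [])
    (hge : stb_vorbis.codebook_count w.mem g.f ≤ (i : Int)) : AtC16 u₀ g w := by
  refine ⟨A, i, hfr, hh, hc.slot_f, ?_, hc.sd4 hno, A2, A3, hc.ages⟩
  have := hc.ages.n_le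
  omega

/-- **The assertion of segment C2 at its inner cut points** (the returns of its calls, before the `lengths` allocation): the common
part, the hand-over carrier, the carried clauses, `temps = []`, `i < count`, and `r14 = c = cb(i)` as a number. `bound`: the
result of the `get_bits` that just returned is below it (`z < 2^n` of the callee's post). -/
structure InC2 (u₀ : State) (g : Ghost) (i : Nat) (A2 A3 : Arena) (A : Arena × List Obj) (pc : Word) (bound : Nat) (v : State) :
    Prop where
  frame : Frame u₀ g pc A v
  hand : g.Hand A
  carry : Carry g i A2 A3 A v.mem
  noTemps : A.1.temps = []
  lt : (i : Int) < stb_vorbis.codebook_count v.mem g.f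
  r14 : v.reg .r14 = addr (g.cb v.mem i)
  rax : (v.reg .rax).toNat < bound

/-- **The head of segment C2** (0x114298 … 0x1142b3 `jle` → `AtC16`; … 0x1142e5 `call get_bits` … 0x1142ea = `cut82`). -/
theorem headC2 {Lay : Layout} (hLay : Lay.hi = 0x1000000) {μ : Microarch} (hμ : UserX.MicroOK μ) {u₀ : State}
    (hcode : HasCodeNat Lay u₀ Vorbis.L.start_decoder.entry Vorbis.Code.code_start_decoder.nat Vorbis.L.start_decoder.size)
    (hld4 : Asan.SmallCheck Lay μ Vorbis.WayInv (Vorbis.CodeOK u₀) [.rax, .rcx, .rdx] 4 Vorbis.L.__asan_load4_noabort.entry)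
    (hld8 : Asan.SmallCheck Lay μ Vorbis.WayInv (Vorbis.CodeOK u₀) [.rax, .rcx, .rdx] 8 Vorbis.L.__asan_load8_noabort.entry)
    (h_get_bits : ∀ (others : List Obj) (frames : List (Nat × FrameLayout)) (Blk : Block → Prop) (len : Nat),
      Calls Lay μ Vorbis.WayInv (Vorbis.conv u₀) Vorbis.L.get_bits.entry (Vorbis.Spec.get_bits.spec others frames Blk len))
    (g : Ghost) (i : Nat) (v : State) (A : Arena × List Obj) (hb : BodyC2 u₀ g i A v) :
    ReachVia Lay μ WayInv v (fun w => AtC16 u₀ g w ∨ ∃ A2 A3, InC2 u₀ g i A2 A3 A Vorbis.L.start_decoder.cut82 256 w) := by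
  have hfr := hb.frame
  have he := hfr.entry
  obtain ⟨A2, A3, hcar⟩ := Carry.of_body hb
  have hno : A.1.temps = [] := hb.sd.noTemps
  v_entry he
  simp only [depth] at he_room he_stack
  have hgb := h_get_bits A.2 g.frames' (g.Blk A) g.len
  have hwhere := f_where hfr hb.hand
  have hRA : g.RA = (g.e.reg .rsp).toNat := rfl
  rw [hRA] at hwhere
  have hcntle := hb.sd.done.upto
  have hF1 := hcar.ages.F1
  have w_rip : v.rip = Vorbis.L.start_decoder.cut81 := hfr.rip
  have hv_rsp : v.reg .rsp = g.e.reg .rsp - 1480 := by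
    rw [hfr.rsp]
    unfold Ghost.R Ghost.RA steady
    have := slot_word (g.e.reg .rsp) 0 (by omega) (by omega)
    simpa using this
  have w_eq : Mem.EqOn Vorbis.L.textLo Vorbis.L.textHi u₀.mem v.mem := hfr.code
  have hdf : v.flags .df = false := (show abiInv _ from hfr.inv).1
  have hmx : v.mxcsr &&& 0x1F80 = 0x1F80 := (show abiInv _ from hfr.inv).2
  have hsse := Vorbis.sseOK_of_abiInv hfr.inv
  have hv_f : v.mem.readLE (g.e.reg .rsp - 1456) 8 = g.f := by
    have := hb.slot_f
    unfold Mem.u64 Ghost.R Ghost.RA steady at this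
    rw [slot_word (g.e.reg .rsp) 0x18 (by omega) (by omega)] at this
    exact this
  have hv_i : v.mem.readLE (g.e.reg .rsp - 1432) 4 = i := by
    have := hb.slot_i
    unfold Mem.u32 Ghost.R Ghost.RA steady at this
    rw [slot_word (g.e.reg .rsp) 0x30 (by omega) (by omega)] at this
    exact this
  have hv_cnt : v.mem.readLE (UInt64.ofNat g.f + 160) 4 = v.mem.u32 (g.f + 160) := by
    unfold Mem.u32 addr
    rw [UInt64.ofNat_add]
    rfl
  have hv_cbs : v.mem.readLE (UInt64.ofNat g.f + 168) 8 = v.mem.u64 (g.f + 168) := by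
    unfold Mem.u64 addr
    rw [UInt64.ofNat_add]
    rfl
  have hl : LiveIn A.2 g.frames' g.f 1808 := hb.hand.obj.mono (sub_frames' g A)
  have hi32 : (BitVec.ofNat 32 i).toInt = (i : Int) := by
    rw [toInt_ofNat32 i (by omega)]
    unfold sint32
    rw [if_pos (by omega)]
  have hcnt32 : (BitVec.ofNat 32 (v.mem.u32 (g.f + 160))).toInt = stb_vorbis.codebook_count v.mem g.f := by
    rw [X86.User.Mem.toInt_ofNat32_u32]
    simp only [vacc, voff]
  u_walk hcode [hμ.vendor] until [Vorbis.L.start_decoder.cut181, Vorbis.L.start_decoder.cut82] span [Vorbis.L.textLo, Vorbis.L.textHi] side (v_side)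
  · -- 0x1142a4 check load4 f+0xa0 (line 3746 `f->codebook_count`): inside `*f`
    have hun : ShadowUntouched v.mem s_1142a4.mem := by v_untouched
    exact hl.accSmall hfr.shadow hun _ 4 (by decide) (by u_omega) (by u_omega)
  · -- 0x1142c5 check load8 f+0xa8 (line 3751 `f->codebooks`): inside `*f`
    have hun : ShadowUntouched v.mem s_1142c5.mem := by v_untouched
    exact hl.accSmall hfr.shadow hun _ 8 (by decide) (by u_omega) (by u_omega)
  · v_inv
  · -- the precondition of get_bits(f, 8) at 0x1142e5
    have hun : ShadowUntouched v.mem s_1142e5.mem := by v_untouched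
    have hrdi : (s_1142e5.reg .rdi).toNat = g.f := by
      rw [w_rdi]
      u_omega
    refine ⟨⟨shadowPre_call hfr ?_ hun, ?_, ?_⟩, ?_⟩
    · rw [w_rsp]
      unfold Ghost.R Ghost.RA steady
      u_omega
    · rw [hrdi]
      exact readerEnv hb.hand hb.sd.env.live
    · rw [hrdi, w_mem]
      exact (Reader.store_off_obj hb.sd.bits _ 8 _ (by u_omega) (by u_omega)).1.bits
    · rw [bitsArg_def, w_rsi]
      decide
  · -- exit at 0x1151bf (line 3746, `count ≤ i`): AtC16
    have hs : Mem.SameExcept [⟨(g.e.reg .rsp).toNat - 1888, (g.e.reg .rsp).toNat - 1480⟩] v.mem s_1142b3.mem := by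
      u_same
    have hbits : Bits (g.Blk A) g.len s_1142b3.mem g.f := by
      rw [w_mem]
      exact (Reader.store_off_obj hb.sd.bits _ 8 _ (by u_omega) (by u_omega)).1.bits
    have hrsp : s_1142b3.reg .rsp = addr g.R := by
      rw [w_rsp, ← hv_rsp, hfr.rsp]
    have hinv : abiInv s_1142b3 := by v_inv
    obtain ⟨hfr', hcar', hobj', _⟩ := stepC (pc' := pc_C16) hfr hb.hand hcar hs (by
      intro s hsm
      rw [List.mem_singleton] at hsm
      subst hsm
      left
      unfold Ghost.R Ghost.RA steady depth
      simp only []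
      omega) w_rip hrsp w_eq hinv hbits
    refine ReachVia.done (Or.inl (Carry.toC16 hfr' hb.hand hcar' hno ?_))
    have ecnt : stb_vorbis.codebook_count s_1142b3.mem g.f = stb_vorbis.codebook_count v.mem g.f := by
      simp only [vacc, voff]
      exact hobj'.i32 160 (by decide)
    rw [ecnt]
    rw [hcnt32, hi32] at hbr_1142b3
    exact hbr_1142b3
  · -- 0x1142ea (`cut82`), after get_bits(f, 8) returned
    have hlt : (i : Int) < stb_vorbis.codebook_count v.mem g.f := by
      rw [hcnt32, hi32] at hbr_1142b3
      omega
    have hrdi : (s_1142e5.reg .rdi).toNat = g.f := by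
      rw [w_rdi_1142e5]
      u_omega
    have harg : bitsArg s_1142e5 = 8 := by
      rw [bitsArg_def, w_rsi_1142e5]
      decide
    have hpost : GetBitsSpecPost (g.Blk A) g.len g.f 8 s_1142e5 s_1142e5r := by
      have := w_post
      simp only [get_bits.spec] at this
      rw [hrdi, harg] at this
      exact this
    v_after_call w_rsp_1142e5 w_mem_1142e5
    have hfN : (UInt64.ofNat g.f).toNat = g.f := by u_omega
    simp only [w_rdi_1142e5, hfN] at w_same
    have hs : Mem.SameExcept [⟨(g.e.reg .rsp).toNat - 1888, (g.e.reg .rsp).toNat - 1480⟩,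
        ⟨g.f + 48, g.f + 56⟩, ⟨g.f + 84, g.f + 96⟩, ⟨g.f + 136, g.f + 144⟩, ⟨g.f + 1484, g.f + 1749⟩,
        ⟨g.f + 1752, g.f + 1784⟩] v.mem s_1142e5r.mem := by
      u_same
    have hrsp : s_1142e5r.reg .rsp = addr g.R := by
      rw [w_rsp, ← hv_rsp, hfr.rsp]
    have hinv : abiInv s_1142e5r := w_inv
    obtain ⟨hfr', hcar', hobj', _⟩ := stepC (pc' := Vorbis.L.start_decoder.cut82) hfr hb.hand hcar hs (by
      intro s hsm
      simp only [List.mem_cons, List.mem_nil_iff, or_false] at hsm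
      unfold OKSpan Ghost.R Ghost.RA steady depth
      rcases hsm with rfl | rfl | rfl | rfl | rfl | rfl <;> simp only [] <;> omega) w_rip hrsp w_eq hinv hpost.bits.bits
    have ecnt : stb_vorbis.codebook_count s_1142e5r.mem g.f = stb_vorbis.codebook_count v.mem g.f := by
      simp only [vacc, voff]
      exact hobj'.i32 160 (by decide)
    have ecbs : stb_vorbis.codebooks s_1142e5r.mem g.f = stb_vorbis.codebooks v.mem g.f := by
      simp only [vacc, voff]
      exact hobj'.u64 168 (by decide)
    refine ReachVia.done (Or.inr ⟨A2, A3, hfr', hb.hand, hcar', hno, by rw [ecnt]; exact hlt, ?_, ?_⟩)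
    · -- r14 = cb(i) = codebooks + 2120·i
      rw [w_r14]
      unfold Ghost.cb stb_vorbis.codebooks_at
      rw [ecbs]
      have e1 : Word.ofBV (BitVec.signExtend 64 (BitVec.ofNat 32 i)) = addr i := by
        apply eq_addr
        rw [toNat_sext32 _ (by rw [toNat_ofNat32 i (by omega)]; omega), toNat_ofNat32 i (by omega)]
      have e2 : stb_vorbis.codebooks v.mem g.f = v.mem.u64 (g.f + 168) := by
        simp only [vacc, voff]
      rw [e1, e2]
      simp only [vfield, voff]
      have e3 : i * 2120 + v.mem.u64 (g.f + 168) = v.mem.u64 (g.f + 168) + 2120 * i := by omega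
      rw [e3]
    · have := hpost.bits.result.2 (by omega)
      omega

/-- **An error exit of segment C2 before the allocation** (`AtERR` with eax = 0): SD.ERR from the carried clauses (`SDw.failed`). -/
theorem Carry.toERR {u₀ : State} {g : Ghost} {i : Nat} {A2 A3 : Arena} {A : Arena × List Obj} {w : State}
    (hfr : Frame u₀ g pc_ERR A w) (hh : g.Hand A) (hc : Carry g i A2 A3 A w.mem)
    (hax : (w.reg .rax).toNat % 2 ^ 32 = 0) : AtERR u₀ g w := by
  have hcm : CommentsOK (g.Blk A) w.mem g.f :=
    CommentsOK.reblk (hc.ages.upTo.own.comment (by omega)) (fun B _ hB => up g A B hB)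
  exact ⟨A, hfr, hh, Or.inl ⟨hax, hc.sdw.failed (by omega) (CommentsOK.h1 hcm)⟩⟩

/-- **Line 3753** (`cut82` 0x1142ea: `cmp al, 0x42 ; jne` ERRSTUB(0x14) at 0x114439 → `AtERR`; else `get_bits(f, 8)` → `cut83` 0x114301). -/
theorem sync1 {Lay : Layout} (hLay : Lay.hi = 0x1000000) {μ : Microarch} (hμ : UserX.MicroOK μ) {u₀ : State}
    (hcode : HasCodeNat Lay u₀ Vorbis.L.start_decoder.entry Vorbis.Code.code_start_decoder.nat Vorbis.L.start_decoder.size)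
    (h_get_bits : ∀ (others : List Obj) (frames : List (Nat × FrameLayout)) (Blk : Block → Prop) (len : Nat),
      Calls Lay μ Vorbis.WayInv (Vorbis.conv u₀) Vorbis.L.get_bits.entry (Vorbis.Spec.get_bits.spec others frames Blk len))
    (h_error : ∀ (others : List Obj) (frames : List (Nat × FrameLayout)),
      Calls Lay μ Vorbis.WayInv (Vorbis.conv u₀) Vorbis.L.error.entry (Vorbis.Spec.error.spec others frames))
    (g : Ghost) (i : Nat) (v : State) (A2 A3 : Arena) (A : Arena × List Obj) (b : Nat)
    (hin : InC2 u₀ g i A2 A3 A Vorbis.L.start_decoder.cut82 b v) :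
    ReachVia Lay μ WayInv v (fun w => AtERR u₀ g w ∨ InC2 u₀ g i A2 A3 A Vorbis.L.start_decoder.cut83 256 w) := by
  have hfr := hin.frame
  have hcar := hin.carry
  have hh := hin.hand
  have he := hfr.entry
  v_entry he
  simp only [depth] at he_room he_stack
  have hgb := h_get_bits A.2 g.frames' (g.Blk A) g.len
  have herr := h_error A.2 g.frames'
  have hwhere := f_where hfr hh
  have hRA : g.RA = (g.e.reg .rsp).toNat := rfl
  rw [hRA] at hwhere
  have w_rip : v.rip = Vorbis.L.start_decoder.cut82 := hfr.rip
  have hv_rsp : v.reg .rsp = g.e.reg .rsp - 1480 := by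
    rw [hfr.rsp]
    unfold Ghost.R Ghost.RA steady
    have := slot_word (g.e.reg .rsp) 0 (by omega) (by omega)
    simpa using this
  have w_eq : Mem.EqOn Vorbis.L.textLo Vorbis.L.textHi u₀.mem v.mem := hfr.code
  have hdf : v.flags .df = false := (show abiInv _ from hfr.inv).1
  have hmx : v.mxcsr &&& 0x1F80 = 0x1F80 := (show abiInv _ from hfr.inv).2
  have hsse := Vorbis.sseOK_of_abiInv hfr.inv
  have hv_f : v.mem.readLE (g.e.reg .rsp - 1456) 8 = g.f := by
    have := hcar.slot_f
    unfold Mem.u64 Ghost.R Ghost.RA steady at this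
    rw [slot_word (g.e.reg .rsp) 0x18 (by omega) (by omega)] at this
    exact this
  have hl : LiveIn A.2 g.frames' g.f 1808 := hh.obj.mono (sub_frames' g A)
  have hfN : (UInt64.ofNat g.f).toNat = g.f := by u_omega
  have hbits0 := hcar.sdw.bits
  u_walk hcode [hμ.vendor] until [Vorbis.L.start_decoder.cut4, Vorbis.L.start_decoder.cut83] span [Vorbis.L.textLo, Vorbis.L.textHi] side (v_side)
  · v_inv
  · -- the precondition of error(f, VORBIS_invalid_setup) at 0x114446
    have hun : ShadowUntouched v.mem s_114446.mem := by v_untouched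
    have hrdi : (s_114446.reg .rdi).toNat = g.f := by
      rw [w_rdi]
      exact hfN
    refine ⟨shadowPre_call hfr ?_ hun, ?_⟩
    · rw [w_rsp]
      unfold Ghost.R Ghost.RA steady
      u_omega
    · rw [hrdi]
      exact hl
  · v_inv
  · -- the precondition of get_bits(f, 8) at 0x1142fc
    have hun : ShadowUntouched v.mem s_1142fc.mem := by v_untouched
    have hrdi : (s_1142fc.reg .rdi).toNat = g.f := by
      rw [w_rdi]
      exact hfN
    refine ⟨⟨shadowPre_call hfr ?_ hun, ?_, ?_⟩, ?_⟩
    · rw [w_rsp]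
      unfold Ghost.R Ghost.RA steady
      u_omega
    · rw [hrdi]
      exact readerEnv hh hcar.sdw.env.live
    · rw [hrdi, w_mem]
      exact (Reader.store_off_obj hbits0 _ 8 _ (by u_omega) (by u_omega)).1.bits
    · rw [bitsArg_def, w_rsi]
      decide
  · -- after error returned (0x11444b `jmp 113b22`): the exit AtERR with eax = 0
    obtain ⟨hrax, hunp, _⟩ := w_post
    v_after_call w_rsp_114446 w_mem_114446
    simp only [w_rdi_114446, hfN, voff] at w_same
    have hs : Mem.SameExcept [⟨(g.e.reg .rsp).toNat - 1888, (g.e.reg .rsp).toNat - 1480⟩,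
        ⟨g.f + 140, g.f + 144⟩] v.mem s_114446r.mem := by
      u_same
    have w_rax : s_114446r.reg .rax = 0 := hrax
    u_walk hcode [hμ.vendor] until [Vorbis.L.start_decoder.cut4] span [Vorbis.L.textLo, Vorbis.L.textHi] side (v_side)
    have hs' : Mem.SameExcept [⟨(g.e.reg .rsp).toNat - 1888, (g.e.reg .rsp).toNat - 1480⟩,
        ⟨g.f + 140, g.f + 144⟩] v.mem s_11444b.mem := by
      rw [w_mem]
      exact hs
    have hrsp : s_11444b.reg .rsp = addr g.R := by
      rw [w_rsp, ← hv_rsp, hfr.rsp]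
    have hinv : abiInv s_11444b := by v_inv
    have hbits : Bits (g.Blk A) g.len s_11444b.mem g.f := by
      apply hbits0.frame_fields
      apply Bits.SameFields.of_sameExcept hs'
      all_goals
        intro s hsm
        simp only [List.mem_cons, List.mem_nil_iff, or_false] at hsm
        rcases hsm with rfl | rfl <;> simp only [] <;> omega
    obtain ⟨hfr', hcar', _, _⟩ := stepC (pc' := pc_ERR) hfr hh hcar hs' (by
      intro s hsm
      simp only [List.mem_cons, List.mem_nil_iff, or_false] at hsm
      unfold OKSpan Ghost.R Ghost.RA steady depth
      rcases hsm with rfl | rfl <;> simp only [] <;> omega) w_rip hrsp w_eq hinv hbits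
    refine ReachVia.done (Or.inl (Carry.toERR hfr' hh hcar' ?_))
    rw [w_rax]
    rfl
  · -- 0x114301 (`cut83`), after get_bits(f, 8) returned
    have hrdi : (s_1142fc.reg .rdi).toNat = g.f := by
      rw [w_rdi_1142fc]
      exact hfN
    have harg : bitsArg s_1142fc = 8 := by
      rw [bitsArg_def, w_rsi_1142fc]
      decide
    have hpost : GetBitsSpecPost (g.Blk A) g.len g.f 8 s_1142fc s_1142fcr := by
      have := w_post
      simp only [get_bits.spec] at this
      rw [hrdi, harg] at this
      exact this
    v_after_call w_rsp_1142fc w_mem_1142fc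
    simp only [w_rdi_1142fc, hfN] at w_same
    have hs : Mem.SameExcept [⟨(g.e.reg .rsp).toNat - 1888, (g.e.reg .rsp).toNat - 1480⟩,
        ⟨g.f + 48, g.f + 56⟩, ⟨g.f + 84, g.f + 96⟩, ⟨g.f + 136, g.f + 144⟩, ⟨g.f + 1484, g.f + 1749⟩,
        ⟨g.f + 1752, g.f + 1784⟩] v.mem s_1142fcr.mem := by
      u_same
    have hrsp : s_1142fcr.reg .rsp = addr g.R := by
      rw [w_rsp, ← hv_rsp, hfr.rsp]
    have hinv : abiInv s_1142fcr := w_inv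
    obtain ⟨hfr', hcar', hobj', _⟩ := stepC (pc' := Vorbis.L.start_decoder.cut83) hfr hh hcar hs (by
      intro s hsm
      simp only [List.mem_cons, List.mem_nil_iff, or_false] at hsm
      unfold OKSpan Ghost.R Ghost.RA steady depth
      rcases hsm with rfl | rfl | rfl | rfl | rfl | rfl <;> simp only [] <;> omega) w_rip hrsp w_eq hinv hpost.bits.bits
    have ecnt : stb_vorbis.codebook_count s_1142fcr.mem g.f = stb_vorbis.codebook_count v.mem g.f := by
      simp only [vacc, voff]
      exact hobj'.i32 160 (by decide)
    have ecbs : stb_vorbis.codebooks s_1142fcr.mem g.f = stb_vorbis.codebooks v.mem g.f := by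
      simp only [vacc, voff]
      exact hobj'.u64 168 (by decide)
    refine ReachVia.done (Or.inr ⟨hfr', hh, hcar', hin.noTemps, by rw [ecnt]; exact hin.lt, ?_, ?_⟩)
    · rw [w_kept .r14 rfl, hin.r14]
      unfold Ghost.cb stb_vorbis.codebooks_at
      rw [ecbs]
    · have := hpost.bits.result.2 (by omega)
      omega

/-- **Line 3754** (`cut83` 0x114301: `cmp al, 0x43 ; jne` ERRSTUB(0x14) at 0x114450 → `AtERR`; else `get_bits(f, 8)` → `cut84` 0x114318). -/
theorem sync2 {Lay : Layout} (hLay : Lay.hi = 0x1000000) {μ : Microarch} (hμ : UserX.MicroOK μ) {u₀ : State}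
    (hcode : HasCodeNat Lay u₀ Vorbis.L.start_decoder.entry Vorbis.Code.code_start_decoder.nat Vorbis.L.start_decoder.size)
    (h_get_bits : ∀ (others : List Obj) (frames : List (Nat × FrameLayout)) (Blk : Block → Prop) (len : Nat),
      Calls Lay μ Vorbis.WayInv (Vorbis.conv u₀) Vorbis.L.get_bits.entry (Vorbis.Spec.get_bits.spec others frames Blk len))
    (h_error : ∀ (others : List Obj) (frames : List (Nat × FrameLayout)),
      Calls Lay μ Vorbis.WayInv (Vorbis.conv u₀) Vorbis.L.error.entry (Vorbis.Spec.error.spec others frames))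
    (g : Ghost) (i : Nat) (v : State) (A2 A3 : Arena) (A : Arena × List Obj) (b : Nat)
    (hin : InC2 u₀ g i A2 A3 A Vorbis.L.start_decoder.cut83 b v) :
    ReachVia Lay μ WayInv v (fun w => AtERR u₀ g w ∨ InC2 u₀ g i A2 A3 A Vorbis.L.start_decoder.cut84 256 w) := by
  have hfr := hin.frame
  have hcar := hin.carry
  have hh := hin.hand
  have he := hfr.entry
  v_entry he
  simp only [depth] at he_room he_stack
  have hgb := h_get_bits A.2 g.frames' (g.Blk A) g.len
  have herr := h_error A.2 g.frames'
  have hwhere := f_where hfr hh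
  have hRA : g.RA = (g.e.reg .rsp).toNat := rfl
  rw [hRA] at hwhere
  have w_rip : v.rip = Vorbis.L.start_decoder.cut83 := hfr.rip
  have hv_rsp : v.reg .rsp = g.e.reg .rsp - 1480 := by
    rw [hfr.rsp]
    unfold Ghost.R Ghost.RA steady
    have := slot_word (g.e.reg .rsp) 0 (by omega) (by omega)
    simpa using this
  have w_eq : Mem.EqOn Vorbis.L.textLo Vorbis.L.textHi u₀.mem v.mem := hfr.code
  have hdf : v.flags .df = false := (show abiInv _ from hfr.inv).1
  have hmx : v.mxcsr &&& 0x1F80 = 0x1F80 := (show abiInv _ from hfr.inv).2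
  have hsse := Vorbis.sseOK_of_abiInv hfr.inv
  have hv_f : v.mem.readLE (g.e.reg .rsp - 1456) 8 = g.f := by
    have := hcar.slot_f
    unfold Mem.u64 Ghost.R Ghost.RA steady at this
    rw [slot_word (g.e.reg .rsp) 0x18 (by omega) (by omega)] at this
    exact this
  have hl : LiveIn A.2 g.frames' g.f 1808 := hh.obj.mono (sub_frames' g A)
  have hfN : (UInt64.ofNat g.f).toNat = g.f := by u_omega
  have hbits0 := hcar.sdw.bits
  u_walk hcode [hμ.vendor] until [Vorbis.L.start_decoder.cut4, Vorbis.L.start_decoder.cut84] span [Vorbis.L.textLo, Vorbis.L.textHi] side (v_side)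
  · v_inv
  · -- the precondition of error(f, VORBIS_invalid_setup) at 0x11445d
    have hun : ShadowUntouched v.mem s_11445d.mem := by v_untouched
    have hrdi : (s_11445d.reg .rdi).toNat = g.f := by
      rw [w_rdi]
      exact hfN
    refine ⟨shadowPre_call hfr ?_ hun, ?_⟩
    · rw [w_rsp]
      unfold Ghost.R Ghost.RA steady
      u_omega
    · rw [hrdi]
      exact hl
  · v_inv
  · -- the precondition of get_bits(f, 8) at 0x114313
    have hun : ShadowUntouched v.mem s_114313.mem := by v_untouched
    have hrdi : (s_114313.reg .rdi).toNat = g.f := by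
      rw [w_rdi]
      exact hfN
    refine ⟨⟨shadowPre_call hfr ?_ hun, ?_, ?_⟩, ?_⟩
    · rw [w_rsp]
      unfold Ghost.R Ghost.RA steady
      u_omega
    · rw [hrdi]
      exact readerEnv hh hcar.sdw.env.live
    · rw [hrdi, w_mem]
      exact (Reader.store_off_obj hbits0 _ 8 _ (by u_omega) (by u_omega)).1.bits
    · rw [bitsArg_def, w_rsi]
      decide
  · -- after error returned (0x114462 `jmp 113b22`): the exit AtERR with eax = 0
    obtain ⟨hrax, hunp, _⟩ := w_post
    v_after_call w_rsp_11445d w_mem_11445d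
    simp only [w_rdi_11445d, hfN, voff] at w_same
    have hs : Mem.SameExcept [⟨(g.e.reg .rsp).toNat - 1888, (g.e.reg .rsp).toNat - 1480⟩,
        ⟨g.f + 140, g.f + 144⟩] v.mem s_11445dr.mem := by
      u_same
    have w_rax : s_11445dr.reg .rax = 0 := hrax
    u_walk hcode [hμ.vendor] until [Vorbis.L.start_decoder.cut4] span [Vorbis.L.textLo, Vorbis.L.textHi] side (v_side)
    have hs' : Mem.SameExcept [⟨(g.e.reg .rsp).toNat - 1888, (g.e.reg .rsp).toNat - 1480⟩,
        ⟨g.f + 140, g.f + 144⟩] v.mem s_114462.mem := by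
      rw [w_mem]
      exact hs
    have hrsp : s_114462.reg .rsp = addr g.R := by
      rw [w_rsp, ← hv_rsp, hfr.rsp]
    have hinv : abiInv s_114462 := by v_inv
    have hbits : Bits (g.Blk A) g.len s_114462.mem g.f := by
      apply hbits0.frame_fields
      apply Bits.SameFields.of_sameExcept hs'
      all_goals
        intro s hsm
        simp only [List.mem_cons, List.mem_nil_iff, or_false] at hsm
        rcases hsm with rfl | rfl <;> simp only [] <;> omega
    obtain ⟨hfr', hcar', _, _⟩ := stepC (pc' := pc_ERR) hfr hh hcar hs' (by
      intro s hsm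
      simp only [List.mem_cons, List.mem_nil_iff, or_false] at hsm
      unfold OKSpan Ghost.R Ghost.RA steady depth
      rcases hsm with rfl | rfl <;> simp only [] <;> omega) w_rip hrsp w_eq hinv hbits
    refine ReachVia.done (Or.inl (Carry.toERR hfr' hh hcar' ?_))
    rw [w_rax]
    rfl
  · -- 0x114301 (`cut84`), after get_bits(f, 8) returned
    have hrdi : (s_114313.reg .rdi).toNat = g.f := by
      rw [w_rdi_114313]
      exact hfN
    have harg : bitsArg s_114313 = 8 := by
      rw [bitsArg_def, w_rsi_114313]
      decide
    have hpost : GetBitsSpecPost (g.Blk A) g.len g.f 8 s_114313 s_114313r := by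
      have := w_post
      simp only [get_bits.spec] at this
      rw [hrdi, harg] at this
      exact this
    v_after_call w_rsp_114313 w_mem_114313
    simp only [w_rdi_114313, hfN] at w_same
    have hs : Mem.SameExcept [⟨(g.e.reg .rsp).toNat - 1888, (g.e.reg .rsp).toNat - 1480⟩,
        ⟨g.f + 48, g.f + 56⟩, ⟨g.f + 84, g.f + 96⟩, ⟨g.f + 136, g.f + 144⟩, ⟨g.f + 1484, g.f + 1749⟩,
        ⟨g.f + 1752, g.f + 1784⟩] v.mem s_114313r.mem := by
      u_same
    have hrsp : s_114313r.reg .rsp = addr g.R := by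
      rw [w_rsp, ← hv_rsp, hfr.rsp]
    have hinv : abiInv s_114313r := w_inv
    obtain ⟨hfr', hcar', hobj', _⟩ := stepC (pc' := Vorbis.L.start_decoder.cut84) hfr hh hcar hs (by
      intro s hsm
      simp only [List.mem_cons, List.mem_nil_iff, or_false] at hsm
      unfold OKSpan Ghost.R Ghost.RA steady depth
      rcases hsm with rfl | rfl | rfl | rfl | rfl | rfl <;> simp only [] <;> omega) w_rip hrsp w_eq hinv hpost.bits.bits
    have ecnt : stb_vorbis.codebook_count s_114313r.mem g.f = stb_vorbis.codebook_count v.mem g.f := by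
      simp only [vacc, voff]
      exact hobj'.i32 160 (by decide)
    have ecbs : stb_vorbis.codebooks s_114313r.mem g.f = stb_vorbis.codebooks v.mem g.f := by
      simp only [vacc, voff]
      exact hobj'.u64 168 (by decide)
    refine ReachVia.done (Or.inr ⟨hfr', hh, hcar', hin.noTemps, by rw [ecnt]; exact hin.lt, ?_, ?_⟩)
    · rw [w_kept .r14 rfl, hin.r14]
      unfold Ghost.cb stb_vorbis.codebooks_at
      rw [ecbs]
    · have := hpost.bits.result.2 (by omega)
      omega

/-- `InC2` from `cut85` on: `r15 = f` besides (loaded at 0x114325 from the spill slot, callee-saved through every call). -/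
structure In15 (u₀ : State) (g : Ghost) (i : Nat) (A2 A3 : Arena) (A : Arena × List Obj) (pc : Word) (bound : Nat) (v : State) :
    Prop extends InC2 u₀ g i A2 A3 A pc bound v where
  r15 : v.reg .r15 = addr g.f

/-- **Lines 3755, 3756** (`cut84` 0x114318: `cmp al, 0x56 ; jne` ERRSTUB(0x14) at 0x114467 → `AtERR`; else `r15 = f`, `get_bits(f, 8)` → `cut85` 0x114332). -/
theorem sync3 {Lay : Layout} (hLay : Lay.hi = 0x1000000) {μ : Microarch} (hμ : UserX.MicroOK μ) {u₀ : State}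
    (hcode : HasCodeNat Lay u₀ Vorbis.L.start_decoder.entry Vorbis.Code.code_start_decoder.nat Vorbis.L.start_decoder.size)
    (h_get_bits : ∀ (others : List Obj) (frames : List (Nat × FrameLayout)) (Blk : Block → Prop) (len : Nat),
      Calls Lay μ Vorbis.WayInv (Vorbis.conv u₀) Vorbis.L.get_bits.entry (Vorbis.Spec.get_bits.spec others frames Blk len))
    (h_error : ∀ (others : List Obj) (frames : List (Nat × FrameLayout)),
      Calls Lay μ Vorbis.WayInv (Vorbis.conv u₀) Vorbis.L.error.entry (Vorbis.Spec.error.spec others frames))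
    (g : Ghost) (i : Nat) (v : State) (A2 A3 : Arena) (A : Arena × List Obj) (b : Nat)
    (hin : InC2 u₀ g i A2 A3 A Vorbis.L.start_decoder.cut84 b v) :
    ReachVia Lay μ WayInv v (fun w => AtERR u₀ g w ∨ In15 u₀ g i A2 A3 A Vorbis.L.start_decoder.cut85 256 w) := by
  have hfr := hin.frame
  have hcar := hin.carry
  have hh := hin.hand
  have he := hfr.entry
  v_entry he
  simp only [depth] at he_room he_stack
  have hgb := h_get_bits A.2 g.frames' (g.Blk A) g.len
  have herr := h_error A.2 g.frames'
  have hwhere := f_where hfr hh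
  have hRA : g.RA = (g.e.reg .rsp).toNat := rfl
  rw [hRA] at hwhere
  have w_rip : v.rip = Vorbis.L.start_decoder.cut84 := hfr.rip
  have hv_rsp : v.reg .rsp = g.e.reg .rsp - 1480 := by
    rw [hfr.rsp]
    unfold Ghost.R Ghost.RA steady
    have := slot_word (g.e.reg .rsp) 0 (by omega) (by omega)
    simpa using this
  have w_eq : Mem.EqOn Vorbis.L.textLo Vorbis.L.textHi u₀.mem v.mem := hfr.code
  have hdf : v.flags .df = false := (show abiInv _ from hfr.inv).1
  have hmx : v.mxcsr &&& 0x1F80 = 0x1F80 := (show abiInv _ from hfr.inv).2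
  have hsse := Vorbis.sseOK_of_abiInv hfr.inv
  have hv_f : v.mem.readLE (g.e.reg .rsp - 1456) 8 = g.f := by
    have := hcar.slot_f
    unfold Mem.u64 Ghost.R Ghost.RA steady at this
    rw [slot_word (g.e.reg .rsp) 0x18 (by omega) (by omega)] at this
    exact this
  have hl : LiveIn A.2 g.frames' g.f 1808 := hh.obj.mono (sub_frames' g A)
  have hfN : (UInt64.ofNat g.f).toNat = g.f := by u_omega
  have hbits0 := hcar.sdw.bits
  u_walk hcode [hμ.vendor] until [Vorbis.L.start_decoder.cut4, Vorbis.L.start_decoder.cut85] span [Vorbis.L.textLo, Vorbis.L.textHi] side (v_side)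
  · v_inv
  · -- the precondition of error(f, VORBIS_invalid_setup) at 0x114474
    have hun : ShadowUntouched v.mem s_114474.mem := by v_untouched
    have hrdi : (s_114474.reg .rdi).toNat = g.f := by
      rw [w_rdi]
      exact hfN
    refine ⟨shadowPre_call hfr ?_ hun, ?_⟩
    · rw [w_rsp]
      unfold Ghost.R Ghost.RA steady
      u_omega
    · rw [hrdi]
      exact hl
  · v_inv
  · -- the precondition of get_bits(f, 8) at 0x11432d
    have hun : ShadowUntouched v.mem s_11432d.mem := by v_untouched
    have hrdi : (s_11432d.reg .rdi).toNat = g.f := by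
      rw [w_rdi]
      exact hfN
    refine ⟨⟨shadowPre_call hfr ?_ hun, ?_, ?_⟩, ?_⟩
    · rw [w_rsp]
      unfold Ghost.R Ghost.RA steady
      u_omega
    · rw [hrdi]
      exact readerEnv hh hcar.sdw.env.live
    · rw [hrdi, w_mem]
      exact (Reader.store_off_obj hbits0 _ 8 _ (by u_omega) (by u_omega)).1.bits
    · rw [bitsArg_def, w_rsi]
      decide
  · -- after error returned (0x114479 `jmp 113b22`): the exit AtERR with eax = 0
    obtain ⟨hrax, hunp, _⟩ := w_post
    v_after_call w_rsp_114474 w_mem_114474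
    simp only [w_rdi_114474, hfN, voff] at w_same
    have hs : Mem.SameExcept [⟨(g.e.reg .rsp).toNat - 1888, (g.e.reg .rsp).toNat - 1480⟩,
        ⟨g.f + 140, g.f + 144⟩] v.mem s_114474r.mem := by
      u_same
    have w_rax : s_114474r.reg .rax = 0 := hrax
    u_walk hcode [hμ.vendor] until [Vorbis.L.start_decoder.cut4] span [Vorbis.L.textLo, Vorbis.L.textHi] side (v_side)
    have hs' : Mem.SameExcept [⟨(g.e.reg .rsp).toNat - 1888, (g.e.reg .rsp).toNat - 1480⟩,
        ⟨g.f + 140, g.f + 144⟩] v.mem s_114479.mem := by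
      rw [w_mem]
      exact hs
    have hrsp : s_114479.reg .rsp = addr g.R := by
      rw [w_rsp, ← hv_rsp, hfr.rsp]
    have hinv : abiInv s_114479 := by v_inv
    have hbits : Bits (g.Blk A) g.len s_114479.mem g.f := by
      apply hbits0.frame_fields
      apply Bits.SameFields.of_sameExcept hs'
      all_goals
        intro s hsm
        simp only [List.mem_cons, List.mem_nil_iff, or_false] at hsm
        rcases hsm with rfl | rfl <;> simp only [] <;> omega
    obtain ⟨hfr', hcar', _, _⟩ := stepC (pc' := pc_ERR) hfr hh hcar hs' (by
      intro s hsm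
      simp only [List.mem_cons, List.mem_nil_iff, or_false] at hsm
      unfold OKSpan Ghost.R Ghost.RA steady depth
      rcases hsm with rfl | rfl <;> simp only [] <;> omega) w_rip hrsp w_eq hinv hbits
    refine ReachVia.done (Or.inl (Carry.toERR hfr' hh hcar' ?_))
    rw [w_rax]
    rfl
  · -- 0x114301 (`cut85`), after get_bits(f, 8) returned
    have hrdi : (s_11432d.reg .rdi).toNat = g.f := by
      rw [w_rdi_11432d]
      exact hfN
    have harg : bitsArg s_11432d = 8 := by
      rw [bitsArg_def, w_rsi_11432d]
      decide
    have hpost : GetBitsSpecPost (g.Blk A) g.len g.f 8 s_11432d s_11432dr := by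
      have := w_post
      simp only [get_bits.spec] at this
      rw [hrdi, harg] at this
      exact this
    v_after_call w_rsp_11432d w_mem_11432d
    simp only [w_rdi_11432d, hfN] at w_same
    have hs : Mem.SameExcept [⟨(g.e.reg .rsp).toNat - 1888, (g.e.reg .rsp).toNat - 1480⟩,
        ⟨g.f + 48, g.f + 56⟩, ⟨g.f + 84, g.f + 96⟩, ⟨g.f + 136, g.f + 144⟩, ⟨g.f + 1484, g.f + 1749⟩,
        ⟨g.f + 1752, g.f + 1784⟩] v.mem s_11432dr.mem := by
      u_same
    have hrsp : s_11432dr.reg .rsp = addr g.R := by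
      rw [w_rsp, ← hv_rsp, hfr.rsp]
    have hinv : abiInv s_11432dr := w_inv
    obtain ⟨hfr', hcar', hobj', _⟩ := stepC (pc' := Vorbis.L.start_decoder.cut85) hfr hh hcar hs (by
      intro s hsm
      simp only [List.mem_cons, List.mem_nil_iff, or_false] at hsm
      unfold OKSpan Ghost.R Ghost.RA steady depth
      rcases hsm with rfl | rfl | rfl | rfl | rfl | rfl <;> simp only [] <;> omega) w_rip hrsp w_eq hinv hpost.bits.bits
    have ecnt : stb_vorbis.codebook_count s_11432dr.mem g.f = stb_vorbis.codebook_count v.mem g.f := by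
      simp only [vacc, voff]
      exact hobj'.i32 160 (by decide)
    have ecbs : stb_vorbis.codebooks s_11432dr.mem g.f = stb_vorbis.codebooks v.mem g.f := by
      simp only [vacc, voff]
      exact hobj'.u64 168 (by decide)
    refine ReachVia.done (Or.inr ⟨⟨hfr', hh, hcar', hin.noTemps, by rw [ecnt]; exact hin.lt, ?_, ?_⟩, by rw [w_r15]; rfl⟩)
    · rw [w_kept .r14 rfl, hin.r14]
      unfold Ghost.cb stb_vorbis.codebooks_at
      rw [ecbs]
    · have := hpost.bits.result.2 (by omega)
      omega

/-- **Line 3757, first half** (`cut85` 0x114332: `mov ebx, eax` (x) ; `get_bits(f, 8)` with `rdi = r15` → `cut86` 0x114341). The value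
of `ebx` is not recorded: only its low byte is used (`movzx ebx, bl`), any byte will do for K1. -/
theorem dims1 {Lay : Layout} (hLay : Lay.hi = 0x1000000) {μ : Microarch} (hμ : UserX.MicroOK μ) {u₀ : State}
    (hcode : HasCodeNat Lay u₀ Vorbis.L.start_decoder.entry Vorbis.Code.code_start_decoder.nat Vorbis.L.start_decoder.size)
    (h_get_bits : ∀ (others : List Obj) (frames : List (Nat × FrameLayout)) (Blk : Block → Prop) (len : Nat),
      Calls Lay μ Vorbis.WayInv (Vorbis.conv u₀) Vorbis.L.get_bits.entry (Vorbis.Spec.get_bits.spec others frames Blk len))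
    (g : Ghost) (i : Nat) (v : State) (A2 A3 : Arena) (A : Arena × List Obj) (b : Nat)
    (hin : In15 u₀ g i A2 A3 A Vorbis.L.start_decoder.cut85 b v) :
    ReachVia Lay μ WayInv v (fun w => In15 u₀ g i A2 A3 A Vorbis.L.start_decoder.cut86 256 w) := by
  have hfr := hin.frame
  have hcar := hin.carry
  have hh := hin.hand
  have he := hfr.entry
  v_entry he
  simp only [depth] at he_room he_stack
  have hgb := h_get_bits A.2 g.frames' (g.Blk A) g.len
  have hwhere := f_where hfr hh
  have hRA : g.RA = (g.e.reg .rsp).toNat := rfl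
  rw [hRA] at hwhere
  have w_rip : v.rip = Vorbis.L.start_decoder.cut85 := hfr.rip
  have hv_rsp : v.reg .rsp = g.e.reg .rsp - 1480 := by
    rw [hfr.rsp]
    unfold Ghost.R Ghost.RA steady
    have := slot_word (g.e.reg .rsp) 0 (by omega) (by omega)
    simpa using this
  have hv_r15 : v.reg .r15 = UInt64.ofNat g.f := hin.r15
  have w_eq : Mem.EqOn Vorbis.L.textLo Vorbis.L.textHi u₀.mem v.mem := hfr.code
  have hdf : v.flags .df = false := (show abiInv _ from hfr.inv).1
  have hmx : v.mxcsr &&& 0x1F80 = 0x1F80 := (show abiInv _ from hfr.inv).2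
  have hsse := Vorbis.sseOK_of_abiInv hfr.inv
  have hfN : (UInt64.ofNat g.f).toNat = g.f := by u_omega
  have hbits0 := hcar.sdw.bits
  u_walk hcode [hμ.vendor] until [Vorbis.L.start_decoder.cut86] span [Vorbis.L.textLo, Vorbis.L.textHi] side (v_side)
  · v_inv
  · -- the precondition of get_bits(f, 8) at 0x11433c
    have hun : ShadowUntouched v.mem s_11433c.mem := by v_untouched
    have hrdi : (s_11433c.reg .rdi).toNat = g.f := by
      rw [w_rdi]
      exact hfN
    refine ⟨⟨shadowPre_call hfr ?_ hun, ?_, ?_⟩, ?_⟩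
    · rw [w_rsp]
      unfold Ghost.R Ghost.RA steady
      u_omega
    · rw [hrdi]
      exact readerEnv hh hcar.sdw.env.live
    · rw [hrdi, w_mem]
      exact (Reader.store_off_obj hbits0 _ 8 _ (by u_omega) (by u_omega)).1.bits
    · rw [bitsArg_def, w_rsi]
      decide
  · -- 0x114341 (`cut86`), after get_bits(f, 8) returned
    have hrdi : (s_11433c.reg .rdi).toNat = g.f := by
      rw [w_rdi_11433c]
      exact hfN
    have harg : bitsArg s_11433c = 8 := by
      rw [bitsArg_def, w_rsi_11433c]
      decide
    have hpost : GetBitsSpecPost (g.Blk A) g.len g.f 8 s_11433c s_11433cr := by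
      have := w_post
      simp only [get_bits.spec] at this
      rw [hrdi, harg] at this
      exact this
    v_after_call w_rsp_11433c w_mem_11433c
    simp only [w_rdi_11433c, hfN] at w_same
    have hs : Mem.SameExcept [⟨(g.e.reg .rsp).toNat - 1888, (g.e.reg .rsp).toNat - 1480⟩,
        ⟨g.f + 48, g.f + 56⟩, ⟨g.f + 84, g.f + 96⟩, ⟨g.f + 136, g.f + 144⟩, ⟨g.f + 1484, g.f + 1749⟩,
        ⟨g.f + 1752, g.f + 1784⟩] v.mem s_11433cr.mem := by
      u_same
    have hrsp : s_11433cr.reg .rsp = addr g.R := by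
      rw [w_rsp, ← hv_rsp, hfr.rsp]
    have hinv : abiInv s_11433cr := w_inv
    obtain ⟨hfr', hcar', hobj', _⟩ := stepC (pc' := Vorbis.L.start_decoder.cut86) hfr hh hcar hs (by
      intro s hsm
      simp only [List.mem_cons, List.mem_nil_iff, or_false] at hsm
      unfold OKSpan Ghost.R Ghost.RA steady depth
      rcases hsm with rfl | rfl | rfl | rfl | rfl | rfl <;> simp only [] <;> omega) w_rip hrsp w_eq hinv hpost.bits.bits
    have ecnt : stb_vorbis.codebook_count s_11433cr.mem g.f = stb_vorbis.codebook_count v.mem g.f := by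
      simp only [vacc, voff]
      exact hobj'.i32 160 (by decide)
    have ecbs : stb_vorbis.codebooks s_11433cr.mem g.f = stb_vorbis.codebooks v.mem g.f := by
      simp only [vacc, voff]
      exact hobj'.u64 168 (by decide)
    refine ReachVia.done ⟨⟨hfr', hh, hcar', hin.noTemps, by rw [ecnt]; exact hin.lt, ?_, ?_⟩, by rw [w_kept .r15 rfl]; exact hin.r15⟩
    · rw [w_kept .r14 rfl, hin.r14]
      unfold Ghost.cb stb_vorbis.codebooks_at
      rw [ecbs]
    · have := hpost.bits.result.2 (by omega)
      omega

/-- **What segment C2 carries once it has stored into the struct `cb(i)`** (from 0x114351 `c->dimensions = …` on): as `Carry`, but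
ZF(i + 1) only, and of the book under construction the bytes the segment never stores — `[c + 8, c + 27)` (`codeword_lengths`,
`minimum_value` … `sequence_p`: the first is stored by the dense allocation, last) and `[c + 28, c + 2120)` — are still zero
(`Fresh7`, `LengthsAt.sparse_null`). -/
structure Carry2 (g : Ghost) (i : Nat) (A2 A3 : Arena) (A : Arena × List Obj) (mem : Mem) : Prop where
  sdw : SDw g.len 3 A (g.Blk A) (g.Live A) mem g.f g.R
  ages : BookTrans A2 A3 A.1 A.1 mem g.f i
  zf : ZF mem (stb_vorbis.codebooks mem g.f) (stb_vorbis.codebook_count mem g.f).toNat (i + 1)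
  slot_f : mem.u64 (g.R + 0x18) = g.f
  slot_i : mem.u32 (g.R + 0x30) = i
  fresh_lo : ZeroFill mem (g.cb mem i + 8) 19
  fresh_hi : ZeroFill mem (g.cb mem i + 28) 2092

/-- The carried clauses at the first store into `cb(i)`: ZF(i) gives ZF(i + 1) and the zero bytes of `cb(i)`. -/
theorem Carry.toCarry2 {g : Ghost} {i : Nat} {A2 A3 : Arena} {A : Arena × List Obj} {mem : Mem}
    (h : Carry g i A2 A3 A mem) (hlt : (i : Int) < stb_vorbis.codebook_count mem g.f) : Carry2 g i A2 A3 A mem := by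
  have hb := h.zf.book i (Nat.le_refl i) (by omega)
  refine ⟨h.sdw, h.ages, ZF.next h.zf, h.slot_f, h.slot_i, ?_, ?_⟩
  · unfold Ghost.cb stb_vorbis.codebooks_at
    intro j hj
    have := hb (8 + j) (by simp only [voff]; omega)
    rw [← Nat.add_assoc] at this
    exact this
  · unfold Ghost.cb stb_vorbis.codebooks_at
    intro j hj
    have := hb (28 + j) (by simp only [voff]; omega)
    rw [← Nat.add_assoc] at this
    exact this

/-- A window of a footprint that the carried clauses tolerate once the struct `cb(i)` (at `c`) is being filled: an `OKSpan`, or inside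
the fields the segment stores — `dimensions`, `entries` (`[c, c + 8)`), `sparse` (`[c + 27, c + 28)`). -/
def OKSpan2 (g : Ghost) (c : Nat) (s : Span) : Prop :=
  OKSpan g s ∨ (c ≤ s.lo ∧ s.hi ≤ c + 8) ∨ (c + 27 ≤ s.lo ∧ s.hi ≤ c + 28)

/-- **ONE STEP OF SEGMENT C2 AFTER THE FIRST STORE INTO `cb(i)`** (as `stepC`, the footprint may also contain stores to the fields
`dimensions`, `entries`, `sparse` of the book under construction): `Frame`, the carried clauses `Carry2` (the record by
`BookTrans.frame`, block by block: the comment blocks are older than the codebooks block, the finished structs are other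
elements of it, their `sorted_values` blocks are younger), and the bytes `[c + 8, c + 27)` read the same. -/
theorem step2 {u₀ : State} {g : Ghost} {pc pc' : Word} {i : Nat} {A2 A3 : Arena} {A : Arena × List Obj} {v w : State}
    (hfr : Frame u₀ g pc A v) (hh : g.Hand A) (hc : Carry2 g i A2 A3 A v.mem)
    (hlt : (i : Int) < stb_vorbis.codebook_count v.mem g.f) {ws : List Span}
    (hs : Mem.SameExcept ws v.mem w.mem) (hws : ∀ s, s ∈ ws → OKSpan2 g (g.cb v.mem i) s)
    (hrip : w.rip = pc') (hrsp : w.reg .rsp = addr g.R) (hcode : CodeOK u₀ w.mem) (hinv : abiInv w)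
    (hbits : Bits (g.Blk A) g.len w.mem g.f) :
    Frame u₀ g pc' A w ∧ Carry2 g i A2 A3 A w.mem ∧ ObjEq carryWins v.mem g.f w.mem g.f ∧
      Mem.EqOn (g.cb v.mem i + 8) (g.cb v.mem i + 27) v.mem w.mem := by
  -- the struct `cb(i)`: inside the codebooks block, a block of the arena
  have hcbok := hc.ages.cbOK
  have hF1 := hc.ages.F1
  have hci := hcbok.cb_in i hlt
  have hcbin := arena_inside hc.sdw.arena hcbok.F2
  have hcboff := hc.sdw.arena.blk_off_stack hcbok.F2
  have hlogout := hh.outside ⟨0x120640, 16⟩ (by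
    simp only [fixedBlocks, globalBlocks, List.mem_cons, true_or, or_true])
  obtain ⟨c, hcdef⟩ : ∃ c, g.cb v.mem i = c := ⟨_, rfl⟩
  rw [hcdef] at hws ⊢
  unfold Ghost.cb at hcdef
  rw [hcdef] at hci
  simp only [vblock, voff] at hci hcbin hcboff hlogout
  obtain ⟨hw1, hw2, hw3⟩ := f_where hfr hh
  obtain ⟨hr1, hr2⟩ := hfr.r_eq
  obtain ⟨ha1, ha2, ha3⟩ := hfr.ra
  simp only [depth, steady] at hr1 ha2
  have harena := hc.sdw.arena
  have hAR1 := harena.AR1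
  have hout := hh.objOut
  simp only [voff] at hout
  -- every window, as arithmetic: off the shadow, off the frame slots, off the arena, off the windows of `*f` that are read
  have hspan : ∀ s, s ∈ ws → s.hi ≤ 0xC00000 ∧
      ((g.RA - 1888 ≤ s.lo ∧ s.hi ≤ g.R) ∨
        (g.f + 48 ≤ s.lo ∧ s.hi ≤ g.f + 56) ∨ (g.f + 84 ≤ s.lo ∧ s.hi ≤ g.f + 96) ∨ (g.f + 136 ≤ s.lo ∧ s.hi ≤ g.f + 144) ∨
        (g.f + 1484 ≤ s.lo ∧ s.hi ≤ g.f + 1749) ∨ (g.f + 1752 ≤ s.lo ∧ s.hi ≤ g.f + 1784) ∨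
        (c ≤ s.lo ∧ s.hi ≤ c + 8) ∨ (c + 27 ≤ s.lo ∧ s.hi ≤ c + 28)) := by
    intro s hsm
    have := hws s hsm
    unfold OKSpan2 OKSpan at this
    simp only [depth] at this
    refine ⟨?_, ?_⟩
    · omega
    · omega
  have hun : Mem.EqOn 0xC00000 0xE00000 v.mem w.mem := by
    apply hs.eqOn
    intro s hsm
    have := (hspan s hsm).1
    omega
  have hslots : Mem.EqOn (g.R + 8) (g.R + 0x38) v.mem w.mem := by
    apply hs.eqOn
    intro s hsm
    have := (hspan s hsm).2
    omega
  have hsaved : Mem.EqOn (g.R + 0x598) (g.R + 0x5d0) v.mem w.mem := by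
    apply hs.eqOn
    intro s hsm
    have := (hspan s hsm).2
    omega
  have hflds : Mem.EqOn (g.f + 112) (g.f + 136) v.mem w.mem := by
    apply hs.eqOn
    intro s hsm
    have := (hspan s hsm).2
    omega
  have hlog : Mem.EqOn 0x120640 0x120650 v.mem w.mem := by
    have hblk : g.Blk A (objBlock g.f) := runBlk_extra List.mem_cons_self
    have hblk2 : g.Blk A ⟨0x120640, 16⟩ := by
      apply runBlk_extra
      simp only [fixedBlocks, globalBlocks, List.mem_cons, true_or, or_true]
    have hd := hc.sdw.env.ok.disjoint hblk hblk2 (by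
      intro e
      have := congrArg Block.size e
      simp only [vblock, voff] at this
      omega)
    simp only [vblock, voff] at hd
    apply hs.eqOn
    intro s hsm
    have := (hspan s hsm).2
    omega
  have hobj : ObjEq carryWins v.mem g.f w.mem g.f := by
    apply ObjEq.of_sameExcept hs
    · intro win hwin
      simp only [carryWins, List.mem_cons, List.mem_nil_iff, or_false] at hwin
      rcases hwin with rfl | rfl | rfl | rfl | rfl <;> simp only [] <;> omega
    · intro win hwin s hsm
      have := (hspan s hsm).2
      simp only [carryWins, List.mem_cons, List.mem_nil_iff, or_false] at hwin
      rcases hwin with rfl | rfl | rfl | rfl | rfl <;> simp only [] <;> omega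
  -- every block of the arena that does not meet `cb(i)` is kept
  have hkeptB : ∀ B, A.1.Blk B → (B.base + B.size ≤ c ∨ c + 28 ≤ B.base) → B.Kept v.mem w.mem := by
    intro B hB hdis
    apply Block.Kept.of_sameExcept hs
    · intro s hsm
      have := (hspan s hsm).2
      have hin := arena_inside harena hB
      have hoff := harena.blk_off_stack hB
      omega
    · exact harena.blkOK.no_wrap hB
  have harena' : ArenaOK A.1 A.2 w.mem g.f := by
    apply harena.frame (by simp only [voff]; omega)
    simp only [voff]
    exact hflds
  have hR64 : g.R + 0x5d0 ≤ 2 ^ 64 := by omega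
  have h3 : A3.Extends A.1 := hc.ages.ext3
  have h2 : A2.Extends A.1 := hc.ages.ext2.trans h3
  have ecnt : stb_vorbis.codebook_count w.mem g.f = stb_vorbis.codebook_count v.mem g.f := by
    simp only [vacc, voff]
    exact hobj.i32 160 (by decide)
  have ecbs : stb_vorbis.codebooks w.mem g.f = stb_vorbis.codebooks v.mem g.f := by
    simp only [vacc, voff]
    exact hobj.u64 168 (by decide)
  have hages : BookTrans A2 A3 A.1 A.1 w.mem g.f i := by
    apply hc.ages.frame (hobj.sub (by decide))
    · -- the comment blocks: blocks of `A2`, the codebooks block was allocated since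
      intro B hR
      have hB : A2.Blk B := hc.ages.comment.reads_blk hR
      have hd := harena.old_disjoint_since h2 hB (hc.ages.F2.mono h3)
      simp only [vblock, voff] at hd
      exact hkeptB B (hB.mono h2) (by omega)
    · -- the structs of the finished books
      intro j hj
      have hlj : (j : Int) < stb_vorbis.codebook_count v.mem g.f := by omega
      have hcj := hcbok.cb_in j hlj
      have hd := CodebooksOK.cb_disjoint v.mem g.f j i (by omega)
      rw [hcdef] at hd
      simp only [vblock, voff] at hcj hd
      apply Block.Kept.of_sameExcept hs
      · intro s hsm
        have := (hspan s hsm).2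
        simp only [vblock, voff]
        omega
      · simp only [vblock, voff]
        omega
    · -- the `sorted_values` blocks of the finished books: allocated since `A3`, the codebooks block is a block of `A3`
      intro j hj hse
      have hS : Since A3 A.1 (Codebook.svBlock v.mem (stb_vorbis.codebooks_at v.mem g.f j)) :=
        (hc.ages.books j hj).K4.sv hse
      generalize Codebook.svBlock v.mem (stb_vorbis.codebooks_at v.mem g.f j) = SB at hS ⊢
      have hd := harena.old_disjoint_since h3 hc.ages.F2.1 hS
      simp only [vblock, voff] at hd
      exact hkeptB SB hS.1 (by omega)
  have hzf : ZF w.mem (stb_vorbis.codebooks w.mem g.f) (stb_vorbis.codebook_count w.mem g.f).toNat (i + 1) := by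
    rw [ecnt, ecbs]
    apply hc.zf.same
    · apply hs.eqOn
      intro s hsm
      have := (hspan s hsm).2
      simp only [stb_vorbis.codebooks_at, voff] at hcdef
      simp only [voff]
      omega
    · omega
    · simp only [voff]
      omega
  have ecb : g.cb w.mem i = c := by
    unfold Ghost.cb stb_vorbis.codebooks_at
    rw [ecbs]
    exact hcdef
  have hlo : Mem.EqOn (c + 8) (c + 27) v.mem w.mem := by
    apply hs.eqOn
    intro s hsm
    have := (hspan s hsm).2
    omega
  have hhi : Mem.EqOn (c + 28) (c + 28 + 2092) v.mem w.mem := by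
    apply hs.eqOn
    intro s hsm
    have := (hspan s hsm).2
    omega
  have hcar' : Carry2 g i A2 A3 A w.mem := by
    refine ⟨sdw_frame hc.sdw (hobj.sub (by decide)) (hslots.mono (Nat.le_refl _) (by omega)) (by omega) hun harena' hbits,
      hages, hzf, ?_, ?_, ?_, ?_⟩
    · rw [hslots.u64 (g.R + 0x18) (by omega) (by omega) (by omega)]
      exact hc.slot_f
    · rw [hslots.u32 (g.R + 0x30) (by omega) (by omega) (by omega)]
      exact hc.slot_i
    · rw [ecb]
      have := hc.fresh_lo
      unfold Ghost.cb at this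
      rw [hcdef] at this
      exact this.same hlo (by omega)
    · rw [ecb]
      have := hc.fresh_hi
      unfold Ghost.cb at this
      rw [hcdef] at this
      exact this.same hhi (by omega)
  refine ⟨?_, hcar', hobj, hlo⟩
  exact
    { entry := hfr.entry
      rip := hrip
      rsp := hrsp
      shadowIdx := by
        rw [hslots.u64 (g.R + 8) (by omega) (by omega) (by omega)]
        exact hfr.shadowIdx
      saved_rbx := by
        rw [hsaved.u64 (g.R + 0x598) (by omega) (by omega) hR64]
        exact hfr.saved_rbx
      saved_rbp := by
        rw [hsaved.u64 (g.R + 0x5a0) (by omega) (by omega) hR64]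
        exact hfr.saved_rbp
      saved_r12 := by
        rw [hsaved.u64 (g.R + 0x5a8) (by omega) (by omega) hR64]
        exact hfr.saved_r12
      saved_r13 := by
        rw [hsaved.u64 (g.R + 0x5b0) (by omega) (by omega) hR64]
        exact hfr.saved_r13
      saved_r14 := by
        rw [hsaved.u64 (g.R + 0x5b8) (by omega) (by omega) hR64]
        exact hfr.saved_r14
      saved_r15 := by
        rw [hsaved.u64 (g.R + 0x5c0) (by omega) (by omega) hR64]
        exact hfr.saved_r15
      saved_ra := by
        rw [hsaved.u64 (g.R + 0x5c8) (by omega) (by omega) hR64]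
        exact hfr.saved_ra
      code := hcode
      inv := hinv
      shadow := hfr.shadow.untouched hun
      offText := hfr.offText
      ext := hfr.ext
      callers := hfr.callers
      sh7 := log2_frame hfr.sh7 hlog
      same := by
        apply hfr.same.step_same hs
        intro s hsm a h1 h2
        have := (hspan s hsm).2
        unfold footprint writes
        have hB0 := hfr.ext.B
        have hL0 := hfr.ext.L
        by_cases hbook : c ≤ s.lo ∧ s.hi ≤ c + 28
        · refine ⟨⟨g.A0.1.B, g.A0.1.B + g.A0.1.L⟩,
            List.mem_cons_of_mem _ (List.mem_cons_of_mem _ (List.mem_cons_of_mem _ List.mem_cons_self)), ?_, ?_⟩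
          · simp only []
            omega
          · simp only []
            omega
        by_cases hst : g.RA - 1888 ≤ s.lo ∧ s.hi ≤ g.R
        · refine ⟨⟨g.RA - depth, g.RA⟩, List.mem_cons_self, ?_, ?_⟩
          · simp only [depth]
            omega
          · simp only []
            omega
        · refine ⟨(objBlock (g.e.reg .rdi).toNat).span, List.mem_cons_of_mem _ List.mem_cons_self, ?_, ?_⟩
          · have e : (g.e.reg .rdi).toNat = g.f := rfl
            simp only [vblock, voff, e]
            omega
          · have e : (g.e.reg .rdi).toNat = g.f := rfl
            simp only [vblock, voff, e]
            omega }

/-- `c->dimensions = (get_bits(f, 8) << 8) + (uint8) x` is at most 65535 (the walker's form of `shl eax, 8 ; movzx ebx, bl ;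
add ebx, eax` with `eax < 256`). -/
theorem dim_bound (x : BitVec 8) (y : BitVec 32) (h : y < 256#32) : BitVec.zeroExtend 32 x + y <<< 8 ≤ 65535#32 := by
  bv_decide

/-- `In15` once the struct `cb(i)` is being filled (from `cut87` on): the carried clauses are `Carry2`; `dimensions` is stored
(two zero-extended bytes: `0 ≤ D ≤ 65535`). -/
structure In2 (u₀ : State) (g : Ghost) (i : Nat) (A2 A3 : Arena) (A : Arena × List Obj) (pc : Word) (bound : Nat) (v : State) :
    Prop where
  frame : Frame u₀ g pc A v
  hand : g.Hand A
  carry : Carry2 g i A2 A3 A v.mem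
  noTemps : A.1.temps = []
  lt : (i : Int) < stb_vorbis.codebook_count v.mem g.f
  r14 : v.reg .r14 = addr (g.cb v.mem i)
  r15 : v.reg .r15 = addr g.f
  rax : (v.reg .rax).toNat < bound
  dim_nonneg : 0 ≤ Codebook.dimensions v.mem (g.cb v.mem i)
  dim_le : Codebook.dimensions v.mem (g.cb v.mem i) ≤ 65535

/-- **Line 3757, second half, and line 3758** (`cut86` 0x114341: `shl eax, 8 ; movzx ebx, bl ; add ebx, eax` ; check store4 `c` ;
`c->dimensions = ebx` ; `get_bits(f, 8)` → `cut87` 0x114361). -/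
theorem dims2 {Lay : Layout} (hLay : Lay.hi = 0x1000000) {μ : Microarch} (hμ : UserX.MicroOK μ) {u₀ : State}
    (hcode : HasCodeNat Lay u₀ Vorbis.L.start_decoder.entry Vorbis.Code.code_start_decoder.nat Vorbis.L.start_decoder.size)
    (hst4 : Asan.SmallCheck Lay μ Vorbis.WayInv (Vorbis.CodeOK u₀) [.rax, .rcx, .rdx] 4 Vorbis.L.__asan_store4_noabort.entry)
    (h_get_bits : ∀ (others : List Obj) (frames : List (Nat × FrameLayout)) (Blk : Block → Prop) (len : Nat),
      Calls Lay μ Vorbis.WayInv (Vorbis.conv u₀) Vorbis.L.get_bits.entry (Vorbis.Spec.get_bits.spec others frames Blk len))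
    (g : Ghost) (i : Nat) (v : State) (A2 A3 : Arena) (A : Arena × List Obj)
    (hin : In15 u₀ g i A2 A3 A Vorbis.L.start_decoder.cut86 256 v) :
    ReachVia Lay μ WayInv v (fun w => In2 u₀ g i A2 A3 A Vorbis.L.start_decoder.cut87 256 w) := by
  have hfr := hin.frame
  have hcar := hin.carry
  have hh := hin.hand
  have he := hfr.entry
  v_entry he
  simp only [depth] at he_room he_stack
  have hgb := h_get_bits A.2 g.frames' (g.Blk A) g.len
  have hwhere := f_where hfr hh
  have hRA : g.RA = (g.e.reg .rsp).toNat := rfl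
  rw [hRA] at hwhere
  have w_rip : v.rip = Vorbis.L.start_decoder.cut86 := hfr.rip
  have hv_rsp : v.reg .rsp = g.e.reg .rsp - 1480 := by
    rw [hfr.rsp]
    unfold Ghost.R Ghost.RA steady
    have := slot_word (g.e.reg .rsp) 0 (by omega) (by omega)
    simpa using this
  have hv_r15 : v.reg .r15 = UInt64.ofNat g.f := hin.r15
  obtain ⟨c, hcdef⟩ : ∃ c, g.cb v.mem i = c := ⟨_, rfl⟩
  have hv_r14 : v.reg .r14 = UInt64.ofNat c := by
    rw [hin.r14, hcdef]
    rfl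
  have w_eq : Mem.EqOn Vorbis.L.textLo Vorbis.L.textHi u₀.mem v.mem := hfr.code
  have hdf : v.flags .df = false := (show abiInv _ from hfr.inv).1
  have hmx : v.mxcsr &&& 0x1F80 = 0x1F80 := (show abiInv _ from hfr.inv).2
  have hsse := Vorbis.sseOK_of_abiInv hfr.inv
  have hfN : (UInt64.ofNat g.f).toNat = g.f := by u_omega
  have hbits0 := hcar.sdw.bits
  -- where the struct is: inside the codebooks block, a live block of the arena, above the text, off the stack, off `*f`
  have hcbok := hcar.ages.cbOK
  have hci := hcbok.cb_in i hin.lt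
  have hcbin := arena_inside hcar.sdw.arena hcbok.F2
  have hcboff := hcar.sdw.arena.blk_off_stack hcbok.F2
  have hAR1 := hcar.sdw.arena.AR1
  have htext := hh.arenaText
  have hout := hh.objOut
  unfold Ghost.cb at hcdef
  rw [hcdef] at hci
  simp only [vblock, voff] at hci hcbin hcboff hout
  have htx : Vorbis.L.textHi = 0x119d40 := rfl
  rw [htx] at htext
  have hcw : 0x119d40 ≤ c ∧ c + 2120 ≤ 0xC00000 ∧ (c + 2120 ≤ 0x700000 ∨ 0x800000 ≤ c) ∧
      (g.f + 1808 ≤ c ∨ c + 2120 ≤ g.f) := by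
    omega
  have hcN : (UInt64.ofNat c).toNat = c := by u_omega
  have hlive : LiveBytes A.2 g.frames' c 2120 := by
    have hbl := hcar.sdw.env.live _ (up g A _ hcbok.F2)
    exact LiveBytes.of_block hbl (by simp only []; omega) (by simp only [voff]; omega)
  u_walk hcode [hμ.vendor] until [Vorbis.L.start_decoder.cut87] span [Vorbis.L.textLo, Vorbis.L.textHi] side (v_side)
  · -- 0x11434c check store4 c (line 3757 `c->dimensions`): inside the codebooks block
    have hun : ShadowUntouched v.mem s_11434c.mem := by v_untouched
    exact hlive.accSmall hfr.shadow hun _ 4 (by decide) (by u_omega) (by u_omega)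
  · v_inv
  · -- the precondition of get_bits(f, 8) at 0x11435c
    have hun : ShadowUntouched v.mem s_11435c.mem := by v_untouched
    have hrdi : (s_11435c.reg .rdi).toNat = g.f := by
      rw [w_rdi]
      exact hfN
    refine ⟨⟨shadowPre_call hfr ?_ hun, ?_, ?_⟩, ?_⟩
    · rw [w_rsp]
      unfold Ghost.R Ghost.RA steady
      u_omega
    · rw [hrdi]
      exact readerEnv hh hcar.sdw.env.live
    · rw [hrdi, w_mem]
      generalize (BitVec.zeroExtend 32 (Word.part Width.w8 (v.reg Reg.rbx)) +
        Word.part Width.w32 (v.reg Reg.rax) <<< 8).toNat = xv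
      have b1 := (Reader.store_off_obj hbits0 (g.e.reg .rsp - 1488) 8 1131345 (by u_omega) (by u_omega)).1.bits
      have b2 := (Reader.store_off_obj b1 (UInt64.ofNat c) 4 xv (by u_omega) (by u_omega)).1.bits
      exact (Reader.store_off_obj b2 (g.e.reg .rsp - 1488) 8 1131361 (by u_omega) (by u_omega)).1.bits
    · rw [bitsArg_def, w_rsi]
      decide
  · -- 0x114361 (`cut87`), after get_bits(f, 8) returned
    have hrdi : (s_11435c.reg .rdi).toNat = g.f := by
      rw [w_rdi_11435c]
      exact hfN
    have harg : bitsArg s_11435c = 8 := by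
      rw [bitsArg_def, w_rsi_11435c]
      decide
    have hpost : GetBitsSpecPost (g.Blk A) g.len g.f 8 s_11435c s_11435cr := by
      have := w_post
      simp only [get_bits.spec] at this
      rw [hrdi, harg] at this
      exact this
    -- the stored `dimensions`, before and after the call
    obtain ⟨D, hDdef⟩ : ∃ D : BitVec 32, BitVec.zeroExtend 32 (Word.part Width.w8 (v.reg Reg.rbx)) +
        Word.part Width.w32 (v.reg Reg.rax) <<< 8 = D := ⟨_, rfl⟩
    have hDle : D.toNat ≤ 65535 := by
      have hy : Word.part Width.w32 (v.reg Reg.rax) < 256#32 := by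
        rw [BitVec.lt_def, Vorbis.toNat_part32]
        have := hin.rax
        show (v.reg Reg.rax).toNat % 2 ^ 32 < 256
        omega
      have := dim_bound (Word.part Width.w8 (v.reg Reg.rbx)) _ hy
      rw [hDdef, BitVec.le_def] at this
      exact this
    rw [hDdef] at w_mem_11435c
    v_after_call w_rsp_11435c w_mem_11435c
    have hD0 : (((v.mem.writeLE (g.e.reg .rsp - 1488) 8 1131345).writeLE (UInt64.ofNat c) 4 D.toNat).writeLE
        (g.e.reg .rsp - 1488) 8 1131361).readLE (UInt64.ofNat c) 4 = D.toNat := by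
      u_read
    simp only [w_rdi_11435c, hfN] at w_same
    have hD1 : s_11435cr.mem.readLE (UInt64.ofNat c) 4 = D.toNat := by
      u_frame hD0
    have hs : Mem.SameExcept [⟨(g.e.reg .rsp).toNat - 1888, (g.e.reg .rsp).toNat - 1480⟩,
        ⟨g.f + 48, g.f + 56⟩, ⟨g.f + 84, g.f + 96⟩, ⟨g.f + 136, g.f + 144⟩, ⟨g.f + 1484, g.f + 1749⟩,
        ⟨g.f + 1752, g.f + 1784⟩, ⟨c, c + 4⟩] v.mem s_11435cr.mem := by
      u_same
    have hrsp : s_11435cr.reg .rsp = addr g.R := by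
      rw [w_rsp, ← hv_rsp, hfr.rsp]
    have hinv : abiInv s_11435cr := w_inv
    have hcb0 : g.cb v.mem i = c := hcdef
    obtain ⟨hfr', hcar', hobj', _⟩ := step2 (pc' := Vorbis.L.start_decoder.cut87) hfr hh (hcar.toCarry2 hin.lt) hin.lt hs (by
      intro s hsm
      rw [hcb0]
      simp only [List.mem_cons, List.mem_nil_iff, or_false] at hsm
      unfold OKSpan2 OKSpan Ghost.R Ghost.RA steady depth
      rcases hsm with rfl | rfl | rfl | rfl | rfl | rfl | rfl <;> simp only [] <;> omega) w_rip hrsp w_eq hinv hpost.bits.bits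
    have ecnt : stb_vorbis.codebook_count s_11435cr.mem g.f = stb_vorbis.codebook_count v.mem g.f := by
      simp only [vacc, voff]
      exact hobj'.i32 160 (by decide)
    have ecbs : stb_vorbis.codebooks s_11435cr.mem g.f = stb_vorbis.codebooks v.mem g.f := by
      simp only [vacc, voff]
      exact hobj'.u64 168 (by decide)
    have ecb : g.cb s_11435cr.mem i = c := by
      unfold Ghost.cb stb_vorbis.codebooks_at
      rw [ecbs]
      exact hcdef
    have hdim : Codebook.dimensions s_11435cr.mem c = (D.toNat : Int) := by
      simp only [vacc, voff]
      unfold Mem.i32 Mem.u32 addr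
      rw [Nat.add_zero, hD1]
      unfold sint32
      rw [if_pos (by omega)]
    refine ReachVia.done ⟨hfr', hh, hcar', hin.noTemps, by rw [ecnt]; exact hin.lt, ?_, ?_, ?_, ?_, ?_⟩
    · rw [w_kept .r14 rfl, hin.r14, ecb]
      unfold Ghost.cb
      rw [hcdef]
    · rw [w_kept .r15 rfl]
      exact hin.r15
    · have := hpost.bits.result.2 (by omega)
      omega
    · rw [ecb, hdim]
      omega
    · rw [ecb, hdim]
      omega

/-- **Line 3759** (`cut87` 0x114361: `mov ebp, eax` (x) ; `get_bits(f, 8)` → `cut88` 0x114370). Only the low byte of `ebp` is used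
later (`movzx ebx, bpl`): its value is not recorded. -/
theorem ent1 {Lay : Layout} (hLay : Lay.hi = 0x1000000) {μ : Microarch} (hμ : UserX.MicroOK μ) {u₀ : State}
    (hcode : HasCodeNat Lay u₀ Vorbis.L.start_decoder.entry Vorbis.Code.code_start_decoder.nat Vorbis.L.start_decoder.size)
    (h_get_bits : ∀ (others : List Obj) (frames : List (Nat × FrameLayout)) (Blk : Block → Prop) (len : Nat),
      Calls Lay μ Vorbis.WayInv (Vorbis.conv u₀) Vorbis.L.get_bits.entry (Vorbis.Spec.get_bits.spec others frames Blk len))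
    (g : Ghost) (i : Nat) (v : State) (A2 A3 : Arena) (A : Arena × List Obj) (b : Nat)
    (hin : In2 u₀ g i A2 A3 A Vorbis.L.start_decoder.cut87 b v) :
    ReachVia Lay μ WayInv v (fun w => In2 u₀ g i A2 A3 A Vorbis.L.start_decoder.cut88 256 w) := by
  have hfr := hin.frame
  have hcar := hin.carry
  have hh := hin.hand
  have he := hfr.entry
  v_entry he
  simp only [depth] at he_room he_stack
  have hgb := h_get_bits A.2 g.frames' (g.Blk A) g.len
  have hwhere := f_where hfr hh
  have hRA : g.RA = (g.e.reg .rsp).toNat := rfl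
  rw [hRA] at hwhere
  have w_rip : v.rip = Vorbis.L.start_decoder.cut87 := hfr.rip
  have hv_rsp : v.reg .rsp = g.e.reg .rsp - 1480 := by
    rw [hfr.rsp]
    unfold Ghost.R Ghost.RA steady
    have := slot_word (g.e.reg .rsp) 0 (by omega) (by omega)
    simpa using this
  have hv_r15 : v.reg .r15 = UInt64.ofNat g.f := hin.r15
  obtain ⟨c, hcdef⟩ : ∃ c, g.cb v.mem i = c := ⟨_, rfl⟩
  have w_eq : Mem.EqOn Vorbis.L.textLo Vorbis.L.textHi u₀.mem v.mem := hfr.code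
  have hdf : v.flags .df = false := (show abiInv _ from hfr.inv).1
  have hmx : v.mxcsr &&& 0x1F80 = 0x1F80 := (show abiInv _ from hfr.inv).2
  have hsse := Vorbis.sseOK_of_abiInv hfr.inv
  have hfN : (UInt64.ofNat g.f).toNat = g.f := by u_omega
  have hbits0 := hcar.sdw.bits
  have hcbok := hcar.ages.cbOK
  have hci := hcbok.cb_in i hin.lt
  have hcbin := arena_inside hcar.sdw.arena hcbok.F2
  have hcboff := hcar.sdw.arena.blk_off_stack hcbok.F2
  have hAR1 := hcar.sdw.arena.AR1
  have hout := hh.objOut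
  have hcb0 : g.cb v.mem i = c := hcdef
  unfold Ghost.cb at hcdef
  rw [hcdef] at hci
  simp only [vblock, voff] at hci hcbin hcboff hout
  have hcw : c + 2120 ≤ 0xC00000 ∧ (c + 2120 ≤ 0x700000 ∨ 0x800000 ≤ c) ∧ (g.f + 1808 ≤ c ∨ c + 2120 ≤ g.f) := by
    omega
  clear hci hcbin hcboff hAR1 hout
  u_walk hcode [hμ.vendor] until [Vorbis.L.start_decoder.cut88] span [Vorbis.L.textLo, Vorbis.L.textHi] side (v_side)
  · v_inv
  · -- the precondition of get_bits(f, 8) at 0x11436b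
    have hun : ShadowUntouched v.mem s_11436b.mem := by v_untouched
    have hrdi : (s_11436b.reg .rdi).toNat = g.f := by
      rw [w_rdi]
      exact hfN
    refine ⟨⟨shadowPre_call hfr ?_ hun, ?_, ?_⟩, ?_⟩
    · rw [w_rsp]
      unfold Ghost.R Ghost.RA steady
      u_omega
    · rw [hrdi]
      exact readerEnv hh hcar.sdw.env.live
    · rw [hrdi, w_mem]
      exact (Reader.store_off_obj hbits0 _ 8 _ (by u_omega) (by u_omega)).1.bits
    · rw [bitsArg_def, w_rsi]
      decide
  · -- 0x114370 (`cut88`), after get_bits(f, 8) returned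
    have hrdi : (s_11436b.reg .rdi).toNat = g.f := by
      rw [w_rdi_11436b]
      exact hfN
    have harg : bitsArg s_11436b = 8 := by
      rw [bitsArg_def, w_rsi_11436b]
      decide
    have hpost : GetBitsSpecPost (g.Blk A) g.len g.f 8 s_11436b s_11436br := by
      have := w_post
      simp only [get_bits.spec] at this
      rw [hrdi, harg] at this
      exact this
    v_after_call w_rsp_11436b w_mem_11436b
    simp only [w_rdi_11436b, hfN] at w_same
    have hs : Mem.SameExcept [⟨(g.e.reg .rsp).toNat - 1888, (g.e.reg .rsp).toNat - 1480⟩,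
        ⟨g.f + 48, g.f + 56⟩, ⟨g.f + 84, g.f + 96⟩, ⟨g.f + 136, g.f + 144⟩, ⟨g.f + 1484, g.f + 1749⟩,
        ⟨g.f + 1752, g.f + 1784⟩] v.mem s_11436br.mem := by
      u_same
    have hrsp : s_11436br.reg .rsp = addr g.R := by
      rw [w_rsp, ← hv_rsp, hfr.rsp]
    have hinv : abiInv s_11436br := w_inv
    obtain ⟨hfr', hcar', hobj', _⟩ := step2 (pc' := Vorbis.L.start_decoder.cut88) hfr hh hcar hin.lt hs (by
      intro s hsm
      rw [hcb0]
      simp only [List.mem_cons, List.mem_nil_iff, or_false] at hsm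
      unfold OKSpan2 OKSpan Ghost.R Ghost.RA steady depth
      rcases hsm with rfl | rfl | rfl | rfl | rfl | rfl <;> simp only [] <;> omega) w_rip hrsp w_eq hinv hpost.bits.bits
    have ecnt : stb_vorbis.codebook_count s_11436br.mem g.f = stb_vorbis.codebook_count v.mem g.f := by
      simp only [vacc, voff]
      exact hobj'.i32 160 (by decide)
    have ecbs : stb_vorbis.codebooks s_11436br.mem g.f = stb_vorbis.codebooks v.mem g.f := by
      simp only [vacc, voff]
      exact hobj'.u64 168 (by decide)
    have ecb : g.cb s_11436br.mem i = c := by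
      unfold Ghost.cb stb_vorbis.codebooks_at
      rw [ecbs]
      exact hcdef
    -- the fields of `cb(i)` stored so far read the same
    have hbook : Mem.EqOn c (c + 8) v.mem s_11436br.mem := by
      apply hs.eqOn
      intro s hsm
      simp only [List.mem_cons, List.mem_nil_iff, or_false] at hsm
      rcases hsm with rfl | rfl | rfl | rfl | rfl | rfl <;> simp only [] <;> omega
    have edim : Codebook.dimensions s_11436br.mem c = Codebook.dimensions v.mem c := by
      simp only [vacc, voff]
      exact hbook.i32 _ (by omega) (by omega) (by omega)
    have hd1 := hin.dim_nonneg
    have hd2 := hin.dim_le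
    rw [hcb0] at hd1 hd2
    refine ReachVia.done ⟨hfr', hh, hcar', hin.noTemps, by rw [ecnt]; exact hin.lt, ?_, ?_, ?_, ?_, ?_⟩
    · rw [w_kept .r14 rfl, hin.r14, ecb, hcb0]
    · rw [w_kept .r15 rfl]
      exact hin.r15
    · have := hpost.bits.result.2 (by omega)
      omega
    · rw [ecb, edim]
      exact hd1
    · rw [ecb, edim]
      exact hd2

/-- **Line 3760, first part** (`cut88` 0x114370: `mov ebx, eax` (y) ; `get_bits(f, 8)` → `cut89` 0x11437f). Only the low byte of `ebx`
is used later (`movzx edx, bl`): its value is not recorded. -/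
theorem ent2 {Lay : Layout} (hLay : Lay.hi = 0x1000000) {μ : Microarch} (hμ : UserX.MicroOK μ) {u₀ : State}
    (hcode : HasCodeNat Lay u₀ Vorbis.L.start_decoder.entry Vorbis.Code.code_start_decoder.nat Vorbis.L.start_decoder.size)
    (h_get_bits : ∀ (others : List Obj) (frames : List (Nat × FrameLayout)) (Blk : Block → Prop) (len : Nat),
      Calls Lay μ Vorbis.WayInv (Vorbis.conv u₀) Vorbis.L.get_bits.entry (Vorbis.Spec.get_bits.spec others frames Blk len))
    (g : Ghost) (i : Nat) (v : State) (A2 A3 : Arena) (A : Arena × List Obj) (b : Nat)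
    (hin : In2 u₀ g i A2 A3 A Vorbis.L.start_decoder.cut88 b v) :
    ReachVia Lay μ WayInv v (fun w => In2 u₀ g i A2 A3 A Vorbis.L.start_decoder.cut89 256 w) := by
  have hfr := hin.frame
  have hcar := hin.carry
  have hh := hin.hand
  have he := hfr.entry
  v_entry he
  simp only [depth] at he_room he_stack
  have hgb := h_get_bits A.2 g.frames' (g.Blk A) g.len
  have hwhere := f_where hfr hh
  have hRA : g.RA = (g.e.reg .rsp).toNat := rfl
  rw [hRA] at hwhere
  have w_rip : v.rip = Vorbis.L.start_decoder.cut88 := hfr.rip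
  have hv_rsp : v.reg .rsp = g.e.reg .rsp - 1480 := by
    rw [hfr.rsp]
    unfold Ghost.R Ghost.RA steady
    have := slot_word (g.e.reg .rsp) 0 (by omega) (by omega)
    simpa using this
  have hv_r15 : v.reg .r15 = UInt64.ofNat g.f := hin.r15
  obtain ⟨c, hcdef⟩ : ∃ c, g.cb v.mem i = c := ⟨_, rfl⟩
  have w_eq : Mem.EqOn Vorbis.L.textLo Vorbis.L.textHi u₀.mem v.mem := hfr.code
  have hdf : v.flags .df = false := (show abiInv _ from hfr.inv).1
  have hmx : v.mxcsr &&& 0x1F80 = 0x1F80 := (show abiInv _ from hfr.inv).2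
  have hsse := Vorbis.sseOK_of_abiInv hfr.inv
  have hfN : (UInt64.ofNat g.f).toNat = g.f := by u_omega
  have hbits0 := hcar.sdw.bits
  have hcbok := hcar.ages.cbOK
  have hci := hcbok.cb_in i hin.lt
  have hcbin := arena_inside hcar.sdw.arena hcbok.F2
  have hcboff := hcar.sdw.arena.blk_off_stack hcbok.F2
  have hAR1 := hcar.sdw.arena.AR1
  have hout := hh.objOut
  have hcb0 : g.cb v.mem i = c := hcdef
  unfold Ghost.cb at hcdef
  rw [hcdef] at hci
  simp only [vblock, voff] at hci hcbin hcboff hout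
  have hcw : c + 2120 ≤ 0xC00000 ∧ (c + 2120 ≤ 0x700000 ∨ 0x800000 ≤ c) ∧ (g.f + 1808 ≤ c ∨ c + 2120 ≤ g.f) := by
    omega
  clear hci hcbin hcboff hAR1 hout
  u_walk hcode [hμ.vendor] until [Vorbis.L.start_decoder.cut89] span [Vorbis.L.textLo, Vorbis.L.textHi] side (v_side)
  · v_inv
  · -- the precondition of get_bits(f, 8) at 0x11437a
    have hun : ShadowUntouched v.mem s_11437a.mem := by v_untouched
    have hrdi : (s_11437a.reg .rdi).toNat = g.f := by
      rw [w_rdi]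
      exact hfN
    refine ⟨⟨shadowPre_call hfr ?_ hun, ?_, ?_⟩, ?_⟩
    · rw [w_rsp]
      unfold Ghost.R Ghost.RA steady
      u_omega
    · rw [hrdi]
      exact readerEnv hh hcar.sdw.env.live
    · rw [hrdi, w_mem]
      exact (Reader.store_off_obj hbits0 _ 8 _ (by u_omega) (by u_omega)).1.bits
    · rw [bitsArg_def, w_rsi]
      decide
  · -- 0x11437f (`cut89`), after get_bits(f, 8) returned
    have hrdi : (s_11437a.reg .rdi).toNat = g.f := by
      rw [w_rdi_11437a]
      exact hfN
    have harg : bitsArg s_11437a = 8 := by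
      rw [bitsArg_def, w_rsi_11437a]
      decide
    have hpost : GetBitsSpecPost (g.Blk A) g.len g.f 8 s_11437a s_11437ar := by
      have := w_post
      simp only [get_bits.spec] at this
      rw [hrdi, harg] at this
      exact this
    v_after_call w_rsp_11437a w_mem_11437a
    simp only [w_rdi_11437a, hfN] at w_same
    have hs : Mem.SameExcept [⟨(g.e.reg .rsp).toNat - 1888, (g.e.reg .rsp).toNat - 1480⟩,
        ⟨g.f + 48, g.f + 56⟩, ⟨g.f + 84, g.f + 96⟩, ⟨g.f + 136, g.f + 144⟩, ⟨g.f + 1484, g.f + 1749⟩,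
        ⟨g.f + 1752, g.f + 1784⟩] v.mem s_11437ar.mem := by
      u_same
    have hrsp : s_11437ar.reg .rsp = addr g.R := by
      rw [w_rsp, ← hv_rsp, hfr.rsp]
    have hinv : abiInv s_11437ar := w_inv
    obtain ⟨hfr', hcar', hobj', _⟩ := step2 (pc' := Vorbis.L.start_decoder.cut89) hfr hh hcar hin.lt hs (by
      intro s hsm
      rw [hcb0]
      simp only [List.mem_cons, List.mem_nil_iff, or_false] at hsm
      unfold OKSpan2 OKSpan Ghost.R Ghost.RA steady depth
      rcases hsm with rfl | rfl | rfl | rfl | rfl | rfl <;> simp only [] <;> omega) w_rip hrsp w_eq hinv hpost.bits.bits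
    have ecnt : stb_vorbis.codebook_count s_11437ar.mem g.f = stb_vorbis.codebook_count v.mem g.f := by
      simp only [vacc, voff]
      exact hobj'.i32 160 (by decide)
    have ecbs : stb_vorbis.codebooks s_11437ar.mem g.f = stb_vorbis.codebooks v.mem g.f := by
      simp only [vacc, voff]
      exact hobj'.u64 168 (by decide)
    have ecb : g.cb s_11437ar.mem i = c := by
      unfold Ghost.cb stb_vorbis.codebooks_at
      rw [ecbs]
      exact hcdef
    -- the fields of `cb(i)` stored so far read the same
    have hbook : Mem.EqOn c (c + 8) v.mem s_11437ar.mem := by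
      apply hs.eqOn
      intro s hsm
      simp only [List.mem_cons, List.mem_nil_iff, or_false] at hsm
      rcases hsm with rfl | rfl | rfl | rfl | rfl | rfl <;> simp only [] <;> omega
    have edim : Codebook.dimensions s_11437ar.mem c = Codebook.dimensions v.mem c := by
      simp only [vacc, voff]
      exact hbook.i32 _ (by omega) (by omega) (by omega)
    have hd1 := hin.dim_nonneg
    have hd2 := hin.dim_le
    rw [hcb0] at hd1 hd2
    refine ReachVia.done ⟨hfr', hh, hcar', hin.noTemps, by rw [ecnt]; exact hin.lt, ?_, ?_, ?_, ?_, ?_⟩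
    · rw [w_kept .r14 rfl, hin.r14, ecb, hcb0]
    · rw [w_kept .r15 rfl]
      exact hin.r15
    · have := hpost.bits.result.2 (by omega)
      omega
    · rw [ecb, edim]
      exact hd1
    · rw [ecb, edim]
      exact hd2

/-- `c->entries = (get_bits(f, 8) << 16) + ((uint8) y << 8) + (uint8) x` is below `2^24` (the walker's form, with `eax < 256`). -/
theorem ent_bound (x y : BitVec 8) (z : BitVec 32) (h : z < 256#32) :
    BitVec.zeroExtend 32 x + (z <<< 16 + BitVec.zeroExtend 32 y <<< 8) < 16777216#32 := by
  bv_decide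

/-- `In2` once `entries` is stored too (from `cut90` on): three zero-extended bytes, `0 ≤ E < 2^24`. -/
structure In3 (u₀ : State) (g : Ghost) (i : Nat) (A2 A3 : Arena) (A : Arena × List Obj) (pc : Word) (bound : Nat) (v : State) :
    Prop extends In2 u₀ g i A2 A3 A pc bound v where
  ent_nonneg : 0 ≤ Codebook.entries v.mem (g.cb v.mem i)
  ent_lt : Codebook.entries v.mem (g.cb v.mem i) < 16777216

/-- **Lines 3760, 3761** (`cut89` 0x11437f: `c->entries = (eax << 16) + ((uint8) y << 8) + (uint8) x` ; check store4 `c + 4` ; the store ;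
`ordered = get_bits(f, 1)` → `cut90` 0x1143aa). -/
theorem ent3 {Lay : Layout} (hLay : Lay.hi = 0x1000000) {μ : Microarch} (hμ : UserX.MicroOK μ) {u₀ : State}
    (hcode : HasCodeNat Lay u₀ Vorbis.L.start_decoder.entry Vorbis.Code.code_start_decoder.nat Vorbis.L.start_decoder.size)
    (hst4 : Asan.SmallCheck Lay μ Vorbis.WayInv (Vorbis.CodeOK u₀) [.rax, .rcx, .rdx] 4 Vorbis.L.__asan_store4_noabort.entry)
    (h_get_bits : ∀ (others : List Obj) (frames : List (Nat × FrameLayout)) (Blk : Block → Prop) (len : Nat),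
      Calls Lay μ Vorbis.WayInv (Vorbis.conv u₀) Vorbis.L.get_bits.entry (Vorbis.Spec.get_bits.spec others frames Blk len))
    (g : Ghost) (i : Nat) (v : State) (A2 A3 : Arena) (A : Arena × List Obj)
    (hin : In2 u₀ g i A2 A3 A Vorbis.L.start_decoder.cut89 256 v) :
    ReachVia Lay μ WayInv v (fun w => In3 u₀ g i A2 A3 A Vorbis.L.start_decoder.cut90 2 w) := by
  have hfr := hin.frame
  have hcar := hin.carry
  have hh := hin.hand
  have he := hfr.entry
  v_entry he
  simp only [depth] at he_room he_stack
  have hgb := h_get_bits A.2 g.frames' (g.Blk A) g.len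
  have hwhere := f_where hfr hh
  have hRA : g.RA = (g.e.reg .rsp).toNat := rfl
  rw [hRA] at hwhere
  have w_rip : v.rip = Vorbis.L.start_decoder.cut89 := hfr.rip
  have hv_rsp : v.reg .rsp = g.e.reg .rsp - 1480 := by
    rw [hfr.rsp]
    unfold Ghost.R Ghost.RA steady
    have := slot_word (g.e.reg .rsp) 0 (by omega) (by omega)
    simpa using this
  have hv_r15 : v.reg .r15 = UInt64.ofNat g.f := hin.r15
  obtain ⟨c, hcdef⟩ : ∃ c, g.cb v.mem i = c := ⟨_, rfl⟩
  have hv_r14 : v.reg .r14 = UInt64.ofNat c := by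
    rw [hin.r14, hcdef]
    rfl
  have w_eq : Mem.EqOn Vorbis.L.textLo Vorbis.L.textHi u₀.mem v.mem := hfr.code
  have hdf : v.flags .df = false := (show abiInv _ from hfr.inv).1
  have hmx : v.mxcsr &&& 0x1F80 = 0x1F80 := (show abiInv _ from hfr.inv).2
  have hsse := Vorbis.sseOK_of_abiInv hfr.inv
  have hfN : (UInt64.ofNat g.f).toNat = g.f := by u_omega
  have hbits0 := hcar.sdw.bits
  -- where the struct is: inside the codebooks block, a live block of the arena, above the text, off the stack, off `*f`
  have hcbok := hcar.ages.cbOK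
  have hci := hcbok.cb_in i hin.lt
  have hcbin := arena_inside hcar.sdw.arena hcbok.F2
  have hcboff := hcar.sdw.arena.blk_off_stack hcbok.F2
  have hAR1 := hcar.sdw.arena.AR1
  have htext := hh.arenaText
  have hout := hh.objOut
  unfold Ghost.cb at hcdef
  rw [hcdef] at hci
  simp only [vblock, voff] at hci hcbin hcboff hout
  have htx : Vorbis.L.textHi = 0x119d40 := rfl
  rw [htx] at htext
  have hcw : 0x119d40 ≤ c ∧ c + 2120 ≤ 0xC00000 ∧ (c + 2120 ≤ 0x700000 ∨ 0x800000 ≤ c) ∧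
      (g.f + 1808 ≤ c ∨ c + 2120 ≤ g.f) := by
    omega
  have hcN : (UInt64.ofNat c).toNat = c := by u_omega
  have hlive : LiveBytes A.2 g.frames' c 2120 := by
    have hbl := hcar.sdw.env.live _ (up g A _ hcbok.F2)
    exact LiveBytes.of_block hbl (by simp only []; omega) (by simp only [voff]; omega)
  u_walk hcode [hμ.vendor] until [Vorbis.L.start_decoder.cut90] span [Vorbis.L.textLo, Vorbis.L.textHi] side (v_side)
  · -- 0x114394 check store4 c+4 (line 3760 `c->entries`): inside the codebooks block
    have hun : ShadowUntouched v.mem s_114394.mem := by v_untouched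
    exact hlive.accSmall hfr.shadow hun _ 4 (by decide) (by u_omega) (by u_omega)
  · v_inv
  · -- the precondition of get_bits(f, 1) at 0x1143a5
    have hun : ShadowUntouched v.mem s_1143a5.mem := by v_untouched
    have hrdi : (s_1143a5.reg .rdi).toNat = g.f := by
      rw [w_rdi]
      exact hfN
    refine ⟨⟨shadowPre_call hfr ?_ hun, ?_, ?_⟩, ?_⟩
    · rw [w_rsp]
      unfold Ghost.R Ghost.RA steady
      u_omega
    · rw [hrdi]
      exact readerEnv hh hcar.sdw.env.live
    · rw [hrdi, w_mem]
      generalize (BitVec.zeroExtend 32 (Word.part Width.w8 (v.reg Reg.rbp)) +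
        (Word.part Width.w32 (v.reg Reg.rax) <<< 16 +
          BitVec.zeroExtend 32 (Word.part Width.w8 (v.reg Reg.rbx)) <<< 8)).toNat = xv
      have b1 := (Reader.store_off_obj hbits0 (g.e.reg .rsp - 1488) 8 1131417 (by u_omega) (by u_omega)).1.bits
      have b2 := (Reader.store_off_obj b1 (UInt64.ofNat c + 4) 4 xv (by u_omega) (by u_omega)).1.bits
      exact (Reader.store_off_obj b2 (g.e.reg .rsp - 1488) 8 1131434 (by u_omega) (by u_omega)).1.bits
    · rw [bitsArg_def, w_rsi]
      decide
  · -- 0x1143aa (`cut90`), after get_bits(f, 1) returned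
    have hrdi : (s_1143a5.reg .rdi).toNat = g.f := by
      rw [w_rdi_1143a5]
      exact hfN
    have harg : bitsArg s_1143a5 = 1 := by
      rw [bitsArg_def, w_rsi_1143a5]
      decide
    have hpost : GetBitsSpecPost (g.Blk A) g.len g.f 1 s_1143a5 s_1143a5r := by
      have := w_post
      simp only [get_bits.spec] at this
      rw [hrdi, harg] at this
      exact this
    -- the stored `entries`, before and after the call
    obtain ⟨E, hEdef⟩ : ∃ E : BitVec 32, BitVec.zeroExtend 32 (Word.part Width.w8 (v.reg Reg.rbp)) +
        (Word.part Width.w32 (v.reg Reg.rax) <<< 16 +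
          BitVec.zeroExtend 32 (Word.part Width.w8 (v.reg Reg.rbx)) <<< 8) = E := ⟨_, rfl⟩
    have hElt : E.toNat < 16777216 := by
      have hy : Word.part Width.w32 (v.reg Reg.rax) < 256#32 := by
        rw [BitVec.lt_def, Vorbis.toNat_part32]
        have := hin.rax
        show (v.reg Reg.rax).toNat % 2 ^ 32 < 256
        omega
      have := ent_bound (Word.part Width.w8 (v.reg Reg.rbp)) (Word.part Width.w8 (v.reg Reg.rbx)) _ hy
      rw [hEdef, BitVec.lt_def] at this
      exact this
    rw [hEdef] at w_mem_1143a5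
    v_after_call w_rsp_1143a5 w_mem_1143a5
    have hE0 : (((v.mem.writeLE (g.e.reg .rsp - 1488) 8 1131417).writeLE (UInt64.ofNat c + 4) 4 E.toNat).writeLE
        (g.e.reg .rsp - 1488) 8 1131434).readLE (UInt64.ofNat c + 4) 4 = E.toNat := by
      u_read
    simp only [w_rdi_1143a5, hfN] at w_same
    have hE1 : s_1143a5r.mem.readLE (UInt64.ofNat c + 4) 4 = E.toNat := by
      u_frame hE0
    have hs : Mem.SameExcept [⟨(g.e.reg .rsp).toNat - 1888, (g.e.reg .rsp).toNat - 1480⟩,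
        ⟨g.f + 48, g.f + 56⟩, ⟨g.f + 84, g.f + 96⟩, ⟨g.f + 136, g.f + 144⟩, ⟨g.f + 1484, g.f + 1749⟩,
        ⟨g.f + 1752, g.f + 1784⟩, ⟨c + 4, c + 8⟩] v.mem s_1143a5r.mem := by
      u_same
    have hrsp : s_1143a5r.reg .rsp = addr g.R := by
      rw [w_rsp, ← hv_rsp, hfr.rsp]
    have hinv : abiInv s_1143a5r := w_inv
    have hcb0 : g.cb v.mem i = c := hcdef
    obtain ⟨hfr', hcar', hobj', _⟩ := step2 (pc' := Vorbis.L.start_decoder.cut90) hfr hh hcar hin.lt hs (by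
      intro s hsm
      rw [hcb0]
      simp only [List.mem_cons, List.mem_nil_iff, or_false] at hsm
      unfold OKSpan2 OKSpan Ghost.R Ghost.RA steady depth
      rcases hsm with rfl | rfl | rfl | rfl | rfl | rfl | rfl <;> simp only [] <;> omega) w_rip hrsp w_eq hinv hpost.bits.bits
    have ecnt : stb_vorbis.codebook_count s_1143a5r.mem g.f = stb_vorbis.codebook_count v.mem g.f := by
      simp only [vacc, voff]
      exact hobj'.i32 160 (by decide)
    have ecbs : stb_vorbis.codebooks s_1143a5r.mem g.f = stb_vorbis.codebooks v.mem g.f := by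
      simp only [vacc, voff]
      exact hobj'.u64 168 (by decide)
    have ecb : g.cb s_1143a5r.mem i = c := by
      unfold Ghost.cb stb_vorbis.codebooks_at
      rw [ecbs]
      exact hcdef
    have hent : Codebook.entries s_1143a5r.mem c = (E.toNat : Int) := by
      simp only [vacc, voff]
      unfold Mem.i32 Mem.u32
      have e4 : addr (c + 4) = UInt64.ofNat c + 4 := by
        unfold addr
        rw [UInt64.ofNat_add]
        rfl
      rw [e4, hE1]
      unfold sint32
      rw [if_pos (by omega)]
    -- `dimensions` reads the same
    have hbook : Mem.EqOn c (c + 4) v.mem s_1143a5r.mem := by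
      apply hs.eqOn
      intro s hsm
      simp only [List.mem_cons, List.mem_nil_iff, or_false] at hsm
      rcases hsm with rfl | rfl | rfl | rfl | rfl | rfl | rfl <;> simp only [] <;> omega
    have edim : Codebook.dimensions s_1143a5r.mem c = Codebook.dimensions v.mem c := by
      simp only [vacc, voff]
      exact hbook.i32 _ (by omega) (by omega) (by omega)
    have hd1 := hin.dim_nonneg
    have hd2 := hin.dim_le
    rw [hcb0] at hd1 hd2
    refine ReachVia.done ⟨⟨hfr', hh, hcar', hin.noTemps, by rw [ecnt]; exact hin.lt, ?_, ?_, ?_, ?_, ?_⟩, ?_, ?_⟩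
    · rw [w_kept .r14 rfl, hin.r14, ecb, hcb0]
    · rw [w_kept .r15 rfl]
      exact hin.r15
    · have := hpost.bits.result.2 (by omega)
      omega
    · rw [ecb, edim]
      exact hd1
    · rw [ecb, edim]
      exact hd2
    · rw [ecb, hent]
      omega
    · rw [ecb, hent]
      omega

/-- **THE FIRST 77 OF THE 129 INSTRUCTIONS OF SEGMENT C2, COMPOSED** (0x114298 … 0x1143aa = `cut90`, with the exit to `AtC16` and the three
ERRSTUBs of lines 3753 – 3755): from the entry assertion `AtC2 i` the machine reaches `AtC16`, `AtERR`, or the inner cut point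
`cut90` (after `ordered = get_bits(f, 1)` returned) with `In3`: `Frame`, the carried clauses `Carry2`, `i < count`, `r14 = cb(i)`,
`r15 = f`, `eax < 2`, `0 ≤ dimensions ≤ 65535`, `0 ≤ entries < 2^24` — the proposed entry assertion of the second sub-segment. -/
theorem to_cut90 {Lay : Layout} (hLay : Lay.hi = 0x1000000) {μ : Microarch} (hμ : UserX.MicroOK μ) {u₀ : State}
    (hcode : HasCodeNat Lay u₀ Vorbis.L.start_decoder.entry Vorbis.Code.code_start_decoder.nat Vorbis.L.start_decoder.size)
    (hld4 : Asan.SmallCheck Lay μ Vorbis.WayInv (Vorbis.CodeOK u₀) [.rax, .rcx, .rdx] 4 Vorbis.L.__asan_load4_noabort.entry)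
    (hld8 : Asan.SmallCheck Lay μ Vorbis.WayInv (Vorbis.CodeOK u₀) [.rax, .rcx, .rdx] 8 Vorbis.L.__asan_load8_noabort.entry)
    (h_get_bits : ∀ (others : List Obj) (frames : List (Nat × FrameLayout)) (Blk : Block → Prop) (len : Nat),
      Calls Lay μ Vorbis.WayInv (Vorbis.conv u₀) Vorbis.L.get_bits.entry (Vorbis.Spec.get_bits.spec others frames Blk len))
    (hst4 : Asan.SmallCheck Lay μ Vorbis.WayInv (Vorbis.CodeOK u₀) [.rax, .rcx, .rdx] 4 Vorbis.L.__asan_store4_noabort.entry)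
    (h_error : ∀ (others : List Obj) (frames : List (Nat × FrameLayout)),
      Calls Lay μ Vorbis.WayInv (Vorbis.conv u₀) Vorbis.L.error.entry (Vorbis.Spec.error.spec others frames))
    (g : Ghost) (i : Nat) (v : State) (hat : AtC2 u₀ g i v) :
    ReachVia Lay μ WayInv v (fun w => AtC16 u₀ g w ∨ AtERR u₀ g w ∨
      ∃ A A2 A3, In3 u₀ g i A2 A3 A Vorbis.L.start_decoder.cut90 2 w) := by
  obtain ⟨A, hb⟩ := hat
  -- 0x114298 … 0x1142ea
  refine (headC2 hLay hμ hcode hld4 hld8 h_get_bits g i v A hb).trans ?_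
  intro v1 h1
  rcases h1 with h16 | ⟨A2, A3, h1⟩
  · exact ReachVia.done (Or.inl h16)
  -- line 3753
  refine (sync1 hLay hμ hcode h_get_bits h_error g i v1 A2 A3 A 256 h1).trans ?_
  intro v2 h2
  rcases h2 with herr | h2
  · exact ReachVia.done (Or.inr (Or.inl herr))
  -- line 3754
  refine (sync2 hLay hμ hcode h_get_bits h_error g i v2 A2 A3 A 256 h2).trans ?_
  intro v3 h3
  rcases h3 with herr | h3
  · exact ReachVia.done (Or.inr (Or.inl herr))
  -- lines 3755, 3756
  refine (sync3 hLay hμ hcode h_get_bits h_error g i v3 A2 A3 A 256 h3).trans ?_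
  intro v4 h4
  rcases h4 with herr | h4
  · exact ReachVia.done (Or.inr (Or.inl herr))
  -- lines 3757, 3758
  refine (dims1 hLay hμ hcode h_get_bits g i v4 A2 A3 A 256 h4).trans ?_
  intro v5 h5
  refine (dims2 hLay hμ hcode hst4 h_get_bits g i v5 A2 A3 A h5).trans ?_
  intro v6 h6
  -- lines 3759 – 3761
  refine (ent1 hLay hμ hcode h_get_bits g i v6 A2 A3 A 256 h6).trans ?_
  intro v7 h7
  refine (ent2 hLay hμ hcode h_get_bits g i v7 A2 A3 A 256 h7).trans ?_
  intro v8 h8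
  refine (ent3 hLay hμ hcode hst4 h_get_bits g i v8 A2 A3 A h8).trans ?_
  intro v9 h9
  exact ReachVia.done (Or.inr (Or.inr ⟨A, A2, A3, h9⟩))

/-- `In3` at the join 0x1143ba … `chk41` (0x1143be, `call __asan_store1_noabort` for `c->sparse`): `r12 = ordered ∈ {0, 1}`,
`rbx = sparse ∈ {0, 1}` (`ordered ≠ 0`: the 0 of Z10), `rdi = c + 27`. -/
structure In4 (u₀ : State) (g : Ghost) (i : Nat) (A2 A3 : Arena) (A : Arena × List Obj) (pc : Word) (v : State) : Prop where
  base : ∃ b, In3 u₀ g i A2 A3 A pc b v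
  ord : ∃ o : Nat, v.reg .r12 = addr o ∧ o < 2 ∧ ∃ s : Nat, v.reg .rbx = addr s ∧ s < 2 ∧ (o ≠ 0 → s = 0)
  rdi : v.reg .rdi = addr (g.cb v.mem i + 27)

/-- `In3` at `cut97` (0x11448d, after the `get_bits(f, 1)` of `sparse` returned on the path `ordered = 0`): `r12 = 0`, `eax < 2`. -/
structure In3z (u₀ : State) (g : Ghost) (i : Nat) (A2 A3 : Arena) (A : Arena × List Obj) (pc : Word) (v : State) : Prop
    extends In3 u₀ g i A2 A3 A pc 2 v where
  r12 : v.reg .r12 = addr 0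

/-- **Line 3762, the dispatch on `ordered`** (`cut90` 0x1143aa: `mov r12d, eax ; test eax, eax ; je`): `ordered ≠ 0` → `ebx = byte [rsp+10H]`
(= 0: Z10 is load-bearing) → the join, stopped at `chk41`; `ordered = 0` → `get_bits(f, 1)` → `cut97`. -/
theorem ord1 {Lay : Layout} (hLay : Lay.hi = 0x1000000) {μ : Microarch} (hμ : UserX.MicroOK μ) {u₀ : State}
    (hcode : HasCodeNat Lay u₀ Vorbis.L.start_decoder.entry Vorbis.Code.code_start_decoder.nat Vorbis.L.start_decoder.size)
    (h_get_bits : ∀ (others : List Obj) (frames : List (Nat × FrameLayout)) (Blk : Block → Prop) (len : Nat),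
      Calls Lay μ Vorbis.WayInv (Vorbis.conv u₀) Vorbis.L.get_bits.entry (Vorbis.Spec.get_bits.spec others frames Blk len))
    (g : Ghost) (i : Nat) (v : State) (A2 A3 : Arena) (A : Arena × List Obj)
    (hin : In3 u₀ g i A2 A3 A Vorbis.L.start_decoder.cut90 2 v) :
    ReachVia Lay μ WayInv v (fun w => In4 u₀ g i A2 A3 A Vorbis.L.start_decoder.chk41 w ∨ In3z u₀ g i A2 A3 A Vorbis.L.start_decoder.cut97 w) := by
  have hfr := hin.frame
  have hcar := hin.carry
  have hh := hin.hand
  have he := hfr.entry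
  v_entry he
  simp only [depth] at he_room he_stack
  have hgb := h_get_bits A.2 g.frames' (g.Blk A) g.len
  have hwhere := f_where hfr hh
  have hRA : g.RA = (g.e.reg .rsp).toNat := rfl
  rw [hRA] at hwhere
  have w_rip : v.rip = Vorbis.L.start_decoder.cut90 := hfr.rip
  have hv_rsp : v.reg .rsp = g.e.reg .rsp - 1480 := by
    rw [hfr.rsp]
    unfold Ghost.R Ghost.RA steady
    have := slot_word (g.e.reg .rsp) 0 (by omega) (by omega)
    simpa using this
  have hv_r15 : v.reg .r15 = UInt64.ofNat g.f := hin.r15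
  obtain ⟨c, hcdef⟩ : ∃ c, g.cb v.mem i = c := ⟨_, rfl⟩
  have w_eq : Mem.EqOn Vorbis.L.textLo Vorbis.L.textHi u₀.mem v.mem := hfr.code
  have hdf : v.flags .df = false := (show abiInv _ from hfr.inv).1
  have hmx : v.mxcsr &&& 0x1F80 = 0x1F80 := (show abiInv _ from hfr.inv).2
  have hsse := Vorbis.sseOK_of_abiInv hfr.inv
  have hfN : (UInt64.ofNat g.f).toNat = g.f := by u_omega
  have hbits0 := hcar.sdw.bits
  have hcbok := hcar.ages.cbOK
  have hci := hcbok.cb_in i hin.lt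
  have hcbin := arena_inside hcar.sdw.arena hcbok.F2
  have hcboff := hcar.sdw.arena.blk_off_stack hcbok.F2
  have hAR1 := hcar.sdw.arena.AR1
  have hout := hh.objOut
  have hcb0 : g.cb v.mem i = c := hcdef
  unfold Ghost.cb at hcdef
  rw [hcdef] at hci
  simp only [vblock, voff] at hci hcbin hcboff hout
  have hcw : c + 2120 ≤ 0xC00000 ∧ (c + 2120 ≤ 0x700000 ∨ 0x800000 ≤ c) ∧ (g.f + 1808 ≤ c ∨ c + 2120 ≤ g.f) := by
    omega
  clear hci hcbin hcboff hAR1 hout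
  have hz10 := hcar.sdw.frame.z10 (by omega)
  have hv_z10 : v.mem.readLE (g.e.reg .rsp - 1464) 1 = 0 := by
    unfold Mem.u8 Ghost.R Ghost.RA steady at hz10
    rw [slot_word (g.e.reg .rsp) 0x10 (by omega) (by omega)] at hz10
    exact hz10
  have hv_f : v.mem.readLE (g.e.reg .rsp - 1456) 8 = g.f := by
    have := hcar.slot_f
    unfold Mem.u64 Ghost.R Ghost.RA steady at this
    rw [slot_word (g.e.reg .rsp) 0x18 (by omega) (by omega)] at this
    exact this
  have hv_r14 : v.reg .r14 = UInt64.ofNat c := by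
    rw [hin.r14, hcb0]
    rfl
  u_walk hcode [hμ.vendor] until [Vorbis.L.start_decoder.chk41, Vorbis.L.start_decoder.cut97] span [Vorbis.L.textLo, Vorbis.L.textHi] side (v_side)
  · v_inv
  · -- the precondition of get_bits(f, 1) at 0x114488
    have hun : ShadowUntouched v.mem s_114488.mem := by v_untouched
    have hrdi : (s_114488.reg .rdi).toNat = g.f := by
      rw [w_rdi]
      exact hfN
    refine ⟨⟨shadowPre_call hfr ?_ hun, ?_, ?_⟩, ?_⟩
    · rw [w_rsp]
      unfold Ghost.R Ghost.RA steady
      u_omega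
    · rw [hrdi]
      exact readerEnv hh hcar.sdw.env.live
    · rw [hrdi, w_mem]
      exact (Reader.store_off_obj hbits0 _ 8 _ (by u_omega) (by u_omega)).1.bits
    · rw [bitsArg_def, w_rsi]
      decide
  · -- 0x11448d (`cut97`), after get_bits(f, 1) returned: `ordered = 0`
    have hrdi : (s_114488.reg .rdi).toNat = g.f := by
      rw [w_rdi_114488]
      exact hfN
    have harg : bitsArg s_114488 = 1 := by
      rw [bitsArg_def, w_rsi_114488]
      decide
    have hpost : GetBitsSpecPost (g.Blk A) g.len g.f 1 s_114488 s_114488r := by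
      have := w_post
      simp only [get_bits.spec] at this
      rw [hrdi, harg] at this
      exact this
    v_after_call w_rsp_114488 w_mem_114488
    simp only [w_rdi_114488, hfN] at w_same
    have hs : Mem.SameExcept [⟨(g.e.reg .rsp).toNat - 1888, (g.e.reg .rsp).toNat - 1480⟩,
        ⟨g.f + 48, g.f + 56⟩, ⟨g.f + 84, g.f + 96⟩, ⟨g.f + 136, g.f + 144⟩, ⟨g.f + 1484, g.f + 1749⟩,
        ⟨g.f + 1752, g.f + 1784⟩] v.mem s_114488r.mem := by
      u_same
    have hrsp : s_114488r.reg .rsp = addr g.R := by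
      rw [w_rsp, ← hv_rsp, hfr.rsp]
    have hinv : abiInv s_114488r := w_inv
    obtain ⟨hfr', hcar', hobj', _⟩ := step2 (pc' := Vorbis.L.start_decoder.cut97) hfr hh hcar hin.lt hs (by
      intro s hsm
      rw [hcb0]
      simp only [List.mem_cons, List.mem_nil_iff, or_false] at hsm
      unfold OKSpan2 OKSpan Ghost.R Ghost.RA steady depth
      rcases hsm with rfl | rfl | rfl | rfl | rfl | rfl <;> simp only [] <;> omega) w_rip hrsp w_eq hinv hpost.bits.bits
    have ecnt : stb_vorbis.codebook_count s_114488r.mem g.f = stb_vorbis.codebook_count v.mem g.f := by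
      simp only [vacc, voff]
      exact hobj'.i32 160 (by decide)
    have ecbs : stb_vorbis.codebooks s_114488r.mem g.f = stb_vorbis.codebooks v.mem g.f := by
      simp only [vacc, voff]
      exact hobj'.u64 168 (by decide)
    have ecb : g.cb s_114488r.mem i = c := by
      unfold Ghost.cb stb_vorbis.codebooks_at
      rw [ecbs]
      exact hcdef
    have hbook : Mem.EqOn c (c + 8) v.mem s_114488r.mem := by
      apply hs.eqOn
      intro s hsm
      simp only [List.mem_cons, List.mem_nil_iff, or_false] at hsm
      rcases hsm with rfl | rfl | rfl | rfl | rfl | rfl <;> simp only [] <;> omega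
    have edim : Codebook.dimensions s_114488r.mem c = Codebook.dimensions v.mem c := by
      simp only [vacc, voff]
      exact hbook.i32 _ (by omega) (by omega) (by omega)
    have eent : Codebook.entries s_114488r.mem c = Codebook.entries v.mem c := by
      simp only [vacc, voff]
      exact hbook.i32 _ (by omega) (by omega) (by omega)
    have hd1 := hin.dim_nonneg
    have hd2 := hin.dim_le
    have he1 := hin.ent_nonneg
    have he2 := hin.ent_lt
    rw [hcb0] at hd1 hd2 he1 he2
    refine ReachVia.done (Or.inr ⟨⟨⟨hfr', hh, hcar', hin.noTemps, by rw [ecnt]; exact hin.lt, ?_, ?_, ?_, ?_, ?_⟩, ?_, ?_⟩, ?_⟩)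
    · rw [w_kept .r14 rfl, hin.r14, ecb, hcb0]
    · rw [w_kept .r15 rfl]
      exact hin.r15
    · have := hpost.bits.result.2 (by omega)
      omega
    · rw [ecb, edim]
      exact hd1
    · rw [ecb, edim]
      exact hd2
    · rw [ecb, eent]
      exact he1
    · rw [ecb, eent]
      exact he2
    · rw [w_r12]
      apply eq_addr
      rw [Vorbis.toNat_ofBV32]
      exact hbr_1143af
  · -- `ordered ≠ 0`: `sparse = 0` from Z10; the join, at `chk41`; the memory is the entry's
    have hs : Mem.SameExcept [] v.mem s_1143ba.mem := by
      rw [w_mem]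
      exact Mem.SameExcept.refl _ _
    have hrsp : s_1143ba.reg .rsp = addr g.R := by
      rw [w_kept .rsp rfl, hfr.rsp]
    have hinv : abiInv s_1143ba := by v_inv
    have hbits : Bits (g.Blk A) g.len s_1143ba.mem g.f := by
      rw [w_mem]
      exact hbits0
    obtain ⟨hfr', hcar', _, _⟩ := step2 (pc' := Vorbis.L.start_decoder.chk41) hfr hh hcar hin.lt hs (by
      intro s hsm
      exact absurd hsm (List.not_mem_nil)) w_rip hrsp w_eq hinv hbits
    have hord : (v.reg .rax).toNat % 2 ^ 32 = 1 := by
      have h1 := hin.rax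
      have h2 : (Word.part Width.w32 (v.reg Reg.rax)).toNat = (v.reg Reg.rax).toNat % 2 ^ 32 := Vorbis.toNat_part32 _
      omega
    refine ReachVia.done (Or.inl ⟨⟨2, ⟨hfr', hh, hcar', hin.noTemps, ?_, ?_, ?_, ?_, ?_, ?_⟩, ?_, ?_⟩, ⟨1, ?_, by omega, 0, ?_, by omega, fun _ => rfl⟩, ?_⟩)
    · rw [w_mem]
      exact hin.lt
    · rw [w_kept .r14 rfl, w_mem]
      exact hin.r14
    · rw [w_kept .r15 rfl]
      exact hin.r15
    · rw [w_kept .rax rfl]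
      exact hin.rax
    · rw [w_mem]
      exact hin.dim_nonneg
    · rw [w_mem]
      exact hin.dim_le
    · rw [w_mem]
      exact hin.ent_nonneg
    · rw [w_mem]
      exact hin.ent_lt
    · rw [w_r12]
      apply eq_addr
      rw [Vorbis.toNat_ofBV32, Vorbis.toNat_part32]
      exact hord
    · rw [w_rbx]
      rfl
    · rw [w_rdi, w_mem, hcb0]
      unfold addr
      rw [UInt64.ofNat_add]
      rfl

/-- **Line 3762, `ordered = 0`** (`cut97` 0x11448d: `mov ebx, eax ; jmp 0x1143ba`; the join, stopped at `chk41`): `sparse = get_bits(f, 1) < 2`. -/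
theorem ord2 {Lay : Layout} (hLay : Lay.hi = 0x1000000) {μ : Microarch} (hμ : UserX.MicroOK μ) {u₀ : State}
    (hcode : HasCodeNat Lay u₀ Vorbis.L.start_decoder.entry Vorbis.Code.code_start_decoder.nat Vorbis.L.start_decoder.size)
    (h_get_bits : ∀ (others : List Obj) (frames : List (Nat × FrameLayout)) (Blk : Block → Prop) (len : Nat),
      Calls Lay μ Vorbis.WayInv (Vorbis.conv u₀) Vorbis.L.get_bits.entry (Vorbis.Spec.get_bits.spec others frames Blk len))
    (g : Ghost) (i : Nat) (v : State) (A2 A3 : Arena) (A : Arena × List Obj)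
    (hin : In3z u₀ g i A2 A3 A Vorbis.L.start_decoder.cut97 v) :
    ReachVia Lay μ WayInv v (fun w => In4 u₀ g i A2 A3 A Vorbis.L.start_decoder.chk41 w) := by
  have hfr := hin.frame
  have hcar := hin.carry
  have hh := hin.hand
  have he := hfr.entry
  v_entry he
  simp only [depth] at he_room he_stack
  have hgb := h_get_bits A.2 g.frames' (g.Blk A) g.len
  have hwhere := f_where hfr hh
  have hRA : g.RA = (g.e.reg .rsp).toNat := rfl
  rw [hRA] at hwhere
  have w_rip : v.rip = Vorbis.L.start_decoder.cut97 := hfr.rip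
  have hv_rsp : v.reg .rsp = g.e.reg .rsp - 1480 := by
    rw [hfr.rsp]
    unfold Ghost.R Ghost.RA steady
    have := slot_word (g.e.reg .rsp) 0 (by omega) (by omega)
    simpa using this
  have hv_r15 : v.reg .r15 = UInt64.ofNat g.f := hin.r15
  obtain ⟨c, hcdef⟩ : ∃ c, g.cb v.mem i = c := ⟨_, rfl⟩
  have w_eq : Mem.EqOn Vorbis.L.textLo Vorbis.L.textHi u₀.mem v.mem := hfr.code
  have hdf : v.flags .df = false := (show abiInv _ from hfr.inv).1
  have hmx : v.mxcsr &&& 0x1F80 = 0x1F80 := (show abiInv _ from hfr.inv).2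
  have hsse := Vorbis.sseOK_of_abiInv hfr.inv
  have hfN : (UInt64.ofNat g.f).toNat = g.f := by u_omega
  have hbits0 := hcar.sdw.bits
  have hcbok := hcar.ages.cbOK
  have hci := hcbok.cb_in i hin.lt
  have hcbin := arena_inside hcar.sdw.arena hcbok.F2
  have hcboff := hcar.sdw.arena.blk_off_stack hcbok.F2
  have hAR1 := hcar.sdw.arena.AR1
  have hout := hh.objOut
  have hcb0 : g.cb v.mem i = c := hcdef
  unfold Ghost.cb at hcdef
  rw [hcdef] at hci
  simp only [vblock, voff] at hci hcbin hcboff hout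
  have hcw : c + 2120 ≤ 0xC00000 ∧ (c + 2120 ≤ 0x700000 ∨ 0x800000 ≤ c) ∧ (g.f + 1808 ≤ c ∨ c + 2120 ≤ g.f) := by
    omega
  clear hci hcbin hcboff hAR1 hout
  have hv_r14 : v.reg .r14 = UInt64.ofNat c := by
    rw [hin.r14, hcb0]
    rfl
  have hv_r12 : v.reg .r12 = addr 0 := hin.r12
  u_walk hcode [hμ.vendor] until [Vorbis.L.start_decoder.chk41] span [Vorbis.L.textLo, Vorbis.L.textHi] side (v_side)
  have hs : Mem.SameExcept [] v.mem s_1143ba.mem := by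
    rw [w_mem]
    exact Mem.SameExcept.refl _ _
  have hrsp : s_1143ba.reg .rsp = addr g.R := by
    rw [w_kept .rsp rfl, hfr.rsp]
  have hinv : abiInv s_1143ba := by v_inv
  have hbits : Bits (g.Blk A) g.len s_1143ba.mem g.f := by
    rw [w_mem]
    exact hbits0
  obtain ⟨hfr', hcar', _, _⟩ := step2 (pc' := Vorbis.L.start_decoder.chk41) hfr hh hcar hin.lt hs (by
    intro s hsm
    exact absurd hsm (List.not_mem_nil)) w_rip hrsp w_eq hinv hbits
  have hsp : (v.reg .rax).toNat % 2 ^ 32 < 2 := by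
    have h1 := hin.rax
    omega
  refine ReachVia.done ⟨⟨2, ⟨hfr', hh, hcar', hin.noTemps, ?_, ?_, ?_, ?_, ?_, ?_⟩, ?_, ?_⟩,
    ⟨0, ?_, by omega, (v.reg .rax).toNat % 2 ^ 32, ?_, hsp, fun h => absurd rfl h⟩, ?_⟩
  · rw [w_mem]
    exact hin.lt
  · rw [w_kept .r14 rfl, w_mem]
    exact hin.r14
  · rw [w_kept .r15 rfl]
    exact hin.r15
  · rw [w_kept .rax rfl]
    exact hin.rax
  · rw [w_mem]
    exact hin.dim_nonneg
  · rw [w_mem]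
    exact hin.dim_le
  · rw [w_mem]
    exact hin.ent_nonneg
  · rw [w_mem]
    exact hin.ent_lt
  · rw [w_kept .r12 rfl]
    exact hin.r12
  · rw [w_rbx]
    apply eq_addr
    rw [Vorbis.toNat_ofBV32, Vorbis.toNat_part32]
  · rw [w_rdi, w_mem, hcb0]
    unfold addr
    rw [UInt64.ofNat_add]
    rfl

/-- An error exit of segment C2 after the first store into `cb(i)` (`AtERR` with eax = 0): SD.ERR from `Carry2` (`SDw.failed`). -/
theorem Carry2.toERR {u₀ : State} {g : Ghost} {i : Nat} {A2 A3 : Arena} {A : Arena × List Obj} {w : State}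
    (hfr : Frame u₀ g pc_ERR A w) (hh : g.Hand A) (hc : Carry2 g i A2 A3 A w.mem)
    (hax : (w.reg .rax).toNat % 2 ^ 32 = 0) : AtERR u₀ g w := by
  have hcm : CommentsOK (g.Blk A) w.mem g.f :=
    CommentsOK.reblk (hc.ages.upTo.own.comment (by omega)) (fun B _ hB => up g A B hB)
  exact ⟨A, hfr, hh, Or.inl ⟨hax, hc.sdw.failed (by omega) (CommentsOK.h1 hcm)⟩⟩

/-- The assertion of segment C2 right before an allocator call (`ret121` 0x1143ea, sparse; `ret130` 0x1144b4, dense): `Frame`, CUR(i) with the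
head-of-iteration snapshot `Ai = A.1`, no temp block, K1 (FIX 6 passed), `sparse = sp` stored, `codeword_lengths` and the seven fresh fields still 0,
`r12 = ordered = o ∈ {0, 1}`, `rbx = sp`, `ordered ≠ 0 → sparse = 0` (Z10). -/
structure In5 (u₀ : State) (g : Ghost) (i : Nat) (A2 A3 : Arena) (A : Arena × List Obj) (pc : Word) (sp o : Nat) (v : State) :
    Prop where
  frame : Frame u₀ g pc A v
  cur : Cur g i A2 A3 A.1 A v
  noTemps : A.1.temps = []
  k1 : Codebook.K1 v.mem (g.cb v.mem i)
  sparse : Codebook.sparse v.mem (g.cb v.mem i) = sp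
  cl0 : Codebook.codeword_lengths v.mem (g.cb v.mem i) = 0
  fresh : Fresh7 v.mem (g.cb v.mem i)
  r12 : v.reg .r12 = addr o
  rbx : v.reg .rbx = addr sp
  o_lt : o < 2
  ord : o ≠ 0 → sp = 0

/-- `In5` from the carried clauses `Carry2` of the new state (pure): `Cur` is `Carry2` + `Hand` + `i < count` + `r14 = cb(i)`; the fresh fields
are the zero bytes `[c + 8, c + 27)`, `[c + 28, c + 2120)` of the struct. -/
theorem In5.build {u₀ : State} {g : Ghost} {i : Nat} {A2 A3 : Arena} {A : Arena × List Obj} {pc : Word} {sp o : Nat} {w : State}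
    (hfr : Frame u₀ g pc A w) (hh : g.Hand A) (hc : Carry2 g i A2 A3 A w.mem) (hnt : A.1.temps = [])
    (hlt : (i : Int) < stb_vorbis.codebook_count w.mem g.f) (hr14 : w.reg .r14 = addr (g.cb w.mem i))
    (hk1 : Codebook.K1 w.mem (g.cb w.mem i)) (hsp : Codebook.sparse w.mem (g.cb w.mem i) = sp)
    (hr12 : w.reg .r12 = addr o) (hrbx : w.reg .rbx = addr sp) (ho : o < 2) (hord : o ≠ 0 → sp = 0) :
    In5 u₀ g i A2 A3 A pc sp o w := by
  have flo := hc.fresh_lo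
  have fhi := hc.fresh_hi
  refine
    { frame := hfr
      cur := ⟨hc.sdw, hh, hc.ages, hc.zf, hlt, hc.slot_f, hc.slot_i, hr14⟩
      noTemps := hnt
      k1 := hk1
      sparse := hsp
      cl0 := ?_
      fresh := ⟨⟨⟨?_, ?_, ?_⟩, ?_, ?_⟩, ?_, ?_⟩
      r12 := hr12
      rbx := hrbx
      o_lt := ho
      ord := hord }
  · simp only [vacc, voff]
    exact flo.ptr _ (by omega) (by omega)
  · simp only [vacc, voff]
    exact flo.u8 _ (by omega) (by omega)
  · simp only [vacc, voff]
    exact fhi.u32 _ (by omega) (by omega)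
  · simp only [vacc, voff]
    exact fhi.ptr _ (by omega) (by omega)
  · simp only [vacc, voff]
    exact fhi.ptr _ (by omega) (by omega)
  · simp only [vacc, voff]
    exact fhi.ptr _ (by omega) (by omega)
  · simp only [vacc, voff]
    exact fhi.ptr _ (by omega) (by omega)
  · simp only [vacc, voff]
    exact fhi.i32 _ (by omega) (by omega)

/-- **`In5` at the return of the check before an allocator call, pure part**: the state `w` differs from the cut point `v` (`In3`) by pushed
return addresses below `R` and the stored byte `c->sparse`; FIX 6 was passed (`dimensions ≠ 0`). -/
theorem In5.of_step {u₀ : State} {g : Ghost} {i : Nat} {A2 A3 : Arena} {A : Arena × List Obj} {pc pc' : Word} {b sp o : Nat}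
    {v w : State} (hin : In3 u₀ g i A2 A3 A pc b v)
    (hs : Mem.SameExcept [⟨(g.e.reg .rsp).toNat - 1888, (g.e.reg .rsp).toNat - 1480⟩,
      ⟨g.cb v.mem i + 27, g.cb v.mem i + 28⟩] v.mem w.mem)
    (hrip : w.rip = pc') (hrsp : w.reg .rsp = addr g.R) (hcode : CodeOK u₀ w.mem) (hinv : abiInv w)
    (hr14 : w.reg .r14 = v.reg .r14) (hdim : Codebook.dimensions v.mem (g.cb v.mem i) ≠ 0)
    (hsp : w.mem.u8 (g.cb v.mem i + 27) = sp)
    (hr12 : w.reg .r12 = addr o) (hrbx : w.reg .rbx = addr sp) (ho : o < 2) (hord : o ≠ 0 → sp = 0) :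
    In5 u₀ g i A2 A3 A pc' sp o w := by
  have hfr := hin.frame
  have hcar := hin.carry
  have hh := hin.hand
  have hwhere := f_where hfr hh
  have hRA : g.RA = (g.e.reg .rsp).toNat := rfl
  rw [hRA] at hwhere
  have hra := hfr.ra
  have hreq := hfr.r_eq
  simp only [steady, depth] at hra hreq
  rw [hRA] at hra hreq
  obtain ⟨c, hcdef⟩ : ∃ c, g.cb v.mem i = c := ⟨_, rfl⟩
  have hcb0 : g.cb v.mem i = c := hcdef
  have hbits0 := hcar.sdw.bits
  have hcbok := hcar.ages.cbOK
  have hci := hcbok.cb_in i hin.lt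
  have hcbin := arena_inside hcar.sdw.arena hcbok.F2
  have hcboff := hcar.sdw.arena.blk_off_stack hcbok.F2
  have hAR1 := hcar.sdw.arena.AR1
  have hout := hh.objOut
  unfold Ghost.cb at hcdef
  rw [hcdef] at hci
  simp only [vblock, voff] at hci hcbin hcboff hout
  have hcw : c + 2120 ≤ 0xC00000 ∧ (c + 2120 ≤ 0x700000 ∨ 0x800000 ≤ c) ∧ (g.f + 1808 ≤ c ∨ c + 2120 ≤ g.f) := by
    omega
  clear hci hcbin hcboff hAR1 hout
  rw [hcb0] at hs hsp hdim
  have hbits : Bits (g.Blk A) g.len w.mem g.f := by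
    apply hbits0.frame_fields
    apply Bits.SameFields.of_sameExcept hs
    all_goals
      intro s hsm
      simp only [List.mem_cons, List.mem_nil_iff, or_false] at hsm
      rcases hsm with rfl | rfl <;> simp only [] <;> omega
  obtain ⟨hfr', hcar', hobj', _⟩ := step2 (pc' := pc') hfr hh hcar hin.lt hs (by
    intro s hsm
    rw [hcb0]
    simp only [List.mem_cons, List.mem_nil_iff, or_false] at hsm
    unfold OKSpan2 OKSpan Ghost.R Ghost.RA steady depth
    rcases hsm with rfl | rfl <;> simp only [] <;> omega) hrip hrsp hcode hinv hbits
  have ecnt : stb_vorbis.codebook_count w.mem g.f = stb_vorbis.codebook_count v.mem g.f := by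
    simp only [vacc, voff]
    exact hobj'.i32 160 (by decide)
  have ecbs : stb_vorbis.codebooks w.mem g.f = stb_vorbis.codebooks v.mem g.f := by
    simp only [vacc, voff]
    exact hobj'.u64 168 (by decide)
  have ecb : g.cb w.mem i = c := by
    unfold Ghost.cb stb_vorbis.codebooks_at
    rw [ecbs]
    exact hcdef
  have hbook : Mem.EqOn c (c + 8) v.mem w.mem := by
    apply hs.eqOn
    intro s hsm
    simp only [List.mem_cons, List.mem_nil_iff, or_false] at hsm
    rcases hsm with rfl | rfl <;> simp only [] <;> omega
  have edim : Codebook.dimensions w.mem c = Codebook.dimensions v.mem c := by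
    simp only [vacc, voff]
    exact hbook.i32 _ (by omega) (by omega) (by omega)
  have eent : Codebook.entries w.mem c = Codebook.entries v.mem c := by
    simp only [vacc, voff]
    exact hbook.i32 _ (by omega) (by omega) (by omega)
  have hd1 := hin.dim_nonneg
  have hd2 := hin.dim_le
  have he1 := hin.ent_nonneg
  have he2 := hin.ent_lt
  rw [hcb0] at hd1 hd2 he1 he2
  apply In5.build hfr' hh hcar' hin.noTemps (by rw [ecnt]; exact hin.lt) _ _ _ hr12 hrbx ho hord
  · rw [hr14, hin.r14, ecb, hcb0]
  · rw [ecb]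
    refine ⟨?_, ?_, ?_, ?_⟩
    · rw [edim]
      omega
    · rw [edim]
      exact hd2
    · rw [eent]
      exact he1
    · rw [eent]
      exact he2
  · rw [ecb]
    simp only [vacc, voff]
    exact hsp
/-- **Lines 3762 – 3769 up to the return of the check before each allocator call** (`chk41` 0x1143be: check store1 `c + 27` ; `c->sparse = bl` ;
check load4 `c` ; FIX 6 `cmp dword [r14], 0 ; je` ERRSTUB(0x14) at 0x114494 → `AtERR` ; `test bl, bl ; je` ; check load4 `c + 4` → `ret121`
0x1143ea (sparse) / `ret130` 0x1144b4 (dense)) with `In5`. -/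
theorem fix6b {Lay : Layout} (hLay : Lay.hi = 0x1000000) {μ : Microarch} (hμ : UserX.MicroOK μ) {u₀ : State}
    (hcode : HasCodeNat Lay u₀ Vorbis.L.start_decoder.entry Vorbis.Code.code_start_decoder.nat Vorbis.L.start_decoder.size)
    (hst1 : Asan.SmallCheck Lay μ Vorbis.WayInv (Vorbis.CodeOK u₀) [.rax, .rdx] 1 Vorbis.L.__asan_store1_noabort.entry)
    (hld4 : Asan.SmallCheck Lay μ Vorbis.WayInv (Vorbis.CodeOK u₀) [.rax, .rcx, .rdx] 4 Vorbis.L.__asan_load4_noabort.entry)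
    (h_error : ∀ (others : List Obj) (frames : List (Nat × FrameLayout)),
      Calls Lay μ Vorbis.WayInv (Vorbis.conv u₀) Vorbis.L.error.entry (Vorbis.Spec.error.spec others frames))
    (h_get_bits : ∀ (others : List Obj) (frames : List (Nat × FrameLayout)) (Blk : Block → Prop) (len : Nat),
      Calls Lay μ Vorbis.WayInv (Vorbis.conv u₀) Vorbis.L.get_bits.entry (Vorbis.Spec.get_bits.spec others frames Blk len))
    (g : Ghost) (i : Nat) (v : State) (A2 A3 : Arena) (A : Arena × List Obj)
    (hin4 : In4 u₀ g i A2 A3 A Vorbis.L.start_decoder.chk41 v) :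
    ReachVia Lay μ WayInv v (fun w => AtERR u₀ g w ∨ (∃ o, In5 u₀ g i A2 A3 A Vorbis.L.start_decoder.ret121 1 o w) ∨
      ∃ o, In5 u₀ g i A2 A3 A Vorbis.L.start_decoder.ret130 0 o w) := by
  obtain ⟨b, hin⟩ := hin4.base
  obtain ⟨o, hr12, ho2, sp, hrbx, hsp2, hosp⟩ := hin4.ord
  have hfr := hin.frame
  have hcar := hin.carry
  have hh := hin.hand
  have he := hfr.entry
  v_entry he
  simp only [depth] at he_room he_stack
  have hgb := h_get_bits A.2 g.frames' (g.Blk A) g.len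
  have hwhere := f_where hfr hh
  have hRA : g.RA = (g.e.reg .rsp).toNat := rfl
  rw [hRA] at hwhere
  have w_rip : v.rip = Vorbis.L.start_decoder.chk41 := hfr.rip
  have hv_rsp : v.reg .rsp = g.e.reg .rsp - 1480 := by
    rw [hfr.rsp]
    unfold Ghost.R Ghost.RA steady
    have := slot_word (g.e.reg .rsp) 0 (by omega) (by omega)
    simpa using this
  have hv_r15 : v.reg .r15 = UInt64.ofNat g.f := hin.r15
  obtain ⟨c, hcdef⟩ : ∃ c, g.cb v.mem i = c := ⟨_, rfl⟩
  have w_eq : Mem.EqOn Vorbis.L.textLo Vorbis.L.textHi u₀.mem v.mem := hfr.code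
  have hdf : v.flags .df = false := (show abiInv _ from hfr.inv).1
  have hmx : v.mxcsr &&& 0x1F80 = 0x1F80 := (show abiInv _ from hfr.inv).2
  have hsse := Vorbis.sseOK_of_abiInv hfr.inv
  have hfN : (UInt64.ofNat g.f).toNat = g.f := by u_omega
  have hbits0 := hcar.sdw.bits
  have hcbok := hcar.ages.cbOK
  have hci := hcbok.cb_in i hin.lt
  have hcbin := arena_inside hcar.sdw.arena hcbok.F2
  have hcboff := hcar.sdw.arena.blk_off_stack hcbok.F2
  have hAR1 := hcar.sdw.arena.AR1
  have hout := hh.objOut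
  have hcb0 : g.cb v.mem i = c := hcdef
  unfold Ghost.cb at hcdef
  rw [hcdef] at hci
  simp only [vblock, voff] at hci hcbin hcboff hout
  have hcw : c + 2120 ≤ 0xC00000 ∧ (c + 2120 ≤ 0x700000 ∨ 0x800000 ≤ c) ∧ (g.f + 1808 ≤ c ∨ c + 2120 ≤ g.f) := by
    omega
  clear hci hcbin hcboff hAR1 hout
  have hv_r14 : v.reg .r14 = UInt64.ofNat c := by
    rw [hin.r14, hcb0]
    rfl
  have hv_r14 : v.reg .r14 = UInt64.ofNat c := by
    rw [hin.r14, hcb0]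
    rfl
  have hv_rdi : v.reg .rdi = UInt64.ofNat c + 27 := by
    rw [hin4.rdi, hcb0]
    unfold addr
    rw [UInt64.ofNat_add]
    rfl
  have hv_rbx : v.reg .rbx = UInt64.ofNat sp := hrbx
  have hv_r12 : v.reg .r12 = UInt64.ofNat o := hr12
  have hv_f : v.mem.readLE (g.e.reg .rsp - 1456) 8 = g.f := by
    have := hcar.slot_f
    unfold Mem.u64 Ghost.R Ghost.RA steady at this
    rw [slot_word (g.e.reg .rsp) 0x18 (by omega) (by omega)] at this
    exact this
  have herr := h_error A.2 g.frames'
  have hl : LiveIn A.2 g.frames' g.f 1808 := hh.obj.mono (sub_frames' g A)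
  have hlive : LiveBytes A.2 g.frames' c 2120 := by
    have hbl := hcar.sdw.env.live _ (up g A _ hcbok.F2)
    have hci' := hcbok.cb_in i hin.lt
    unfold Ghost.cb at hcb0
    rw [hcb0] at hci'
    simp only [vblock, voff] at hci'
    exact LiveBytes.of_block hbl (by simp only []; omega) (by simp only [voff]; omega)
  have hcN : (UInt64.ofNat c).toNat = c := by u_omega
  have hcw2 : 0x119d40 ≤ c := by
    have := hlive.where_ hfr.shadow hfr.offText (by omega) (by have := hfr.r_eq; have := hfr.ra; unfold steady depth at *; omega)
    omega
  u_walk hcode [hμ.vendor] until [Vorbis.L.start_decoder.cut4, Vorbis.L.start_decoder.ret121, Vorbis.L.start_decoder.ret130] span [Vorbis.L.textLo, Vorbis.L.textHi] side (v_side)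
  · -- 0x1143be check store1 c+27 (line 3762 `c->sparse`)
    have hun : ShadowUntouched v.mem s_1143be.mem := by v_untouched
    exact hlive.accSmall hfr.shadow hun _ 1 (by decide) (by u_omega) (by u_omega)
  · -- 0x1143ca check load4 c (line 3764 `c->dimensions`)
    have hun : ShadowUntouched v.mem s_1143ca.mem := by v_untouched
    exact hlive.accSmall hfr.shadow hun _ 4 (by decide) (by u_omega) (by u_omega)
  · v_inv
  · -- the precondition of error(f, VORBIS_invalid_setup) at 0x1144a1 (FIX 6)
    have hun : ShadowUntouched v.mem s_1144a1.mem := by v_untouched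
    have hrdi : (s_1144a1.reg .rdi).toNat = g.f := by
      rw [w_rdi]
      exact hfN
    refine ⟨shadowPre_call hfr ?_ hun, ?_⟩
    · rw [w_rsp]
      unfold Ghost.R Ghost.RA steady
      u_omega
    · rw [hrdi]
      exact hl
  · -- 0x1144af check load4 c+4 (line 3769 `c->entries`, dense)
    have hun : ShadowUntouched v.mem s_1144af.mem := by v_untouched
    exact hlive.accSmall hfr.shadow hun _ 4 (by decide) (by u_omega) (by u_omega)
  · -- 0x1143e5 check load4 c+4 (line 3767 `c->entries`, sparse)
    have hun : ShadowUntouched v.mem s_1143e5.mem := by v_untouched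
    exact hlive.accSmall hfr.shadow hun _ 4 (by decide) (by u_omega) (by u_omega)
  · -- after error returned (0x1144a6 `jmp 113b22`): the exit AtERR with eax = 0 (FIX 6: `dimensions = 0`)
    obtain ⟨hrax, hunp, _⟩ := w_post
    v_after_call w_rsp_1144a1 w_mem_1144a1
    simp only [w_rdi_1144a1, hfN, voff] at w_same
    have hs : Mem.SameExcept [⟨(g.e.reg .rsp).toNat - 1888, (g.e.reg .rsp).toNat - 1480⟩,
        ⟨g.f + 140, g.f + 144⟩, ⟨c + 27, c + 28⟩] v.mem s_1144a1r.mem := by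
      u_same
    have w_rax : s_1144a1r.reg .rax = 0 := hrax
    u_walk hcode [hμ.vendor] until [Vorbis.L.start_decoder.cut4] span [Vorbis.L.textLo, Vorbis.L.textHi] side (v_side)
    have hs' : Mem.SameExcept [⟨(g.e.reg .rsp).toNat - 1888, (g.e.reg .rsp).toNat - 1480⟩,
        ⟨g.f + 140, g.f + 144⟩, ⟨c + 27, c + 28⟩] v.mem s_1144a6.mem := by
      rw [w_mem]
      exact hs
    have hrsp : s_1144a6.reg .rsp = addr g.R := by
      rw [w_rsp, ← hv_rsp, hfr.rsp]
    have hinv : abiInv s_1144a6 := by v_inv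
    have hbits : Bits (g.Blk A) g.len s_1144a6.mem g.f := by
      apply hbits0.frame_fields
      apply Bits.SameFields.of_sameExcept hs'
      all_goals
        intro s hsm
        simp only [List.mem_cons, List.mem_nil_iff, or_false] at hsm
        rcases hsm with rfl | rfl | rfl <;> simp only [] <;> omega
    obtain ⟨hfr', hcar', _, _⟩ := step2 (pc' := pc_ERR) hfr hh hcar hin.lt hs' (by
      intro s hsm
      rw [hcb0]
      simp only [List.mem_cons, List.mem_nil_iff, or_false] at hsm
      unfold OKSpan2 OKSpan Ghost.R Ghost.RA steady depth
      rcases hsm with rfl | rfl | rfl <;> simp only [] <;> omega) w_rip hrsp w_eq hinv hbits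
    refine ReachVia.done (Or.inl (Carry2.toERR hfr' hh hcar' ?_))
    rw [w_rax]
    rfl
  · -- `ret130`: the check of `c->entries` returned; the exit `In5` (sparse = 0)
    have hs : Mem.SameExcept [⟨(g.e.reg .rsp).toNat - 1888, (g.e.reg .rsp).toNat - 1480⟩, ⟨c + 27, c + 28⟩]
        v.mem s_1144afr.mem := by
      u_same
    have hrsp : s_1144afr.reg .rsp = addr g.R := by
      rw [w_rsp, ← hv_rsp, hfr.rsp]
    have hinv : abiInv s_1144afr := by v_inv
    have hpart : (Word.part Width.w8 (addr sp)).toNat = sp := by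
      rw [Vorbis.Spec.Segment.part8_addr sp (by omega), BitVec.toNat_ofNat]
      exact Nat.mod_eq_of_lt (show sp < 2 ^ 8 by omega)
    rw [hpart] at w_mem hbr_1143db
    have hsp0 : sp = 0 := by omega
    have hspb : s_1144afr.mem.u8 (c + 27) = sp := by
      unfold Mem.u8
      have e27 : addr (c + 27) = UInt64.ofNat c + 27 := by
        unfold addr
        rw [UInt64.ofNat_add]
        rfl
      rw [e27, w_mem]
      u_read
    have hdim : Codebook.dimensions v.mem (g.cb v.mem i) ≠ 0 := by
      rw [hcb0]
      simp only [vacc, voff]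
      unfold Mem.i32 Mem.u32
      have e0 : addr (c + 0) = UInt64.ofNat c := rfl
      rw [e0]
      have hlt := Mem.readLE_lt' v.mem (UInt64.ofNat c) 4
      have hcs := sint32_cases (v.mem.readLE (UInt64.ofNat c) 4)
      omega
    rw [← hcb0] at hs hspb
    have h5 := In5.of_step (pc' := Vorbis.L.start_decoder.ret130) hin hs w_rip hrsp w_eq hinv (w_kept .r14 rfl) hdim hspb
      (by rw [w_kept .r12 rfl]; exact hr12) (by rw [w_kept .rbx rfl]; exact hrbx) ho2 hosp
    rw [hsp0] at h5
    exact ReachVia.done (Or.inr (Or.inr ⟨o, h5⟩))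
  · -- `ret121`: the check of `c->entries` returned; the exit `In5` (sparse = 1)
    have hs : Mem.SameExcept [⟨(g.e.reg .rsp).toNat - 1888, (g.e.reg .rsp).toNat - 1480⟩, ⟨c + 27, c + 28⟩]
        v.mem s_1143e5r.mem := by
      u_same
    have hrsp : s_1143e5r.reg .rsp = addr g.R := by
      rw [w_rsp, ← hv_rsp, hfr.rsp]
    have hinv : abiInv s_1143e5r := by v_inv
    have hpart : (Word.part Width.w8 (addr sp)).toNat = sp := by
      rw [Vorbis.Spec.Segment.part8_addr sp (by omega), BitVec.toNat_ofNat]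
      exact Nat.mod_eq_of_lt (show sp < 2 ^ 8 by omega)
    rw [hpart] at w_mem hbr_1143db
    have hsp0 : sp = 1 := by omega
    have hspb : s_1143e5r.mem.u8 (c + 27) = sp := by
      unfold Mem.u8
      have e27 : addr (c + 27) = UInt64.ofNat c + 27 := by
        unfold addr
        rw [UInt64.ofNat_add]
        rfl
      rw [e27, w_mem]
      u_read
    have hdim : Codebook.dimensions v.mem (g.cb v.mem i) ≠ 0 := by
      rw [hcb0]
      simp only [vacc, voff]
      unfold Mem.i32 Mem.u32
      have e0 : addr (c + 0) = UInt64.ofNat c := rfl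
      rw [e0]
      have hlt := Mem.readLE_lt' v.mem (UInt64.ofNat c) 4
      have hcs := sint32_cases (v.mem.readLE (UInt64.ofNat c) 4)
      omega
    rw [← hcb0] at hs hspb
    have h5 := In5.of_step (pc' := Vorbis.L.start_decoder.ret121) hin hs w_rip hrsp w_eq hinv (w_kept .r14 rfl) hdim hspb
      (by rw [w_kept .r12 rfl]; exact hr12) (by rw [w_kept .rbx rfl]; exact hrbx) ho2 hosp
    rw [hsp0] at h5
    exact ReachVia.done (Or.inr (Or.inl ⟨o, h5⟩))

/-- The assertion of segment C2 at the return of an allocator (`cut91` 0x1143f8, sparse; `cut99` 0x1144c2, dense) and after it: `Frame` and CUR(i)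
for the ghost arena `A'` after the call, the clauses of `In5` about the struct `cb(i)` (no allocator writes it). What the allocator returned is
stated next to it. -/
structure In6 (u₀ : State) (g : Ghost) (i : Nat) (A2 A3 Ai : Arena) (A' : Arena × List Obj) (pc : Word) (sp o : Nat) (v : State) :
    Prop where
  frame : Frame u₀ g pc A' v
  cur : Cur g i A2 A3 Ai A' v
  k1 : Codebook.K1 v.mem (g.cb v.mem i)
  sparse : Codebook.sparse v.mem (g.cb v.mem i) = sp
  cl0 : Codebook.codeword_lengths v.mem (g.cb v.mem i) = 0
  fresh : Fresh7 v.mem (g.cb v.mem i)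
  r12 : v.reg .r12 = addr o
  o_lt : o < 2
  ord : o ≠ 0 → sp = 0

/-- **`In6` from the return of an allocator, pure part**: `Frame` and `Cur` at the returned state `w` for the ghost `A'` (what `Cur.alloc_call`,
`Cur.alloc_fail_any`, `Cur.free` return), `cb(i)` unmoved, every setup block of `A` kept — so the struct reads the same. -/
theorem In6.build {u₀ : State} {g : Ghost} {i : Nat} {A2 A3 : Arena} {A A' : Arena × List Obj} {pc pc' : Word} {sp o : Nat}
    {v w : State} (h : In5 u₀ g i A2 A3 A pc sp o v) (hF : Frame u₀ g pc' A' w) (hC : Cur g i A2 A3 A.1 A' w)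
    (hcb : g.cb w.mem i = g.cb v.mem i) (hkept : AllKept A.1.Blk v.mem w.mem) (hr12 : w.reg .r12 = v.reg .r12) :
    In6 u₀ g i A2 A3 A.1 A' pc' sp o w ∧
      Codebook.entries w.mem (g.cb w.mem i) = Codebook.entries v.mem (g.cb v.mem i) := by
  have hcbOK := h.cur.ages.cbOK
  have hstruct : (Codebook.block (g.cb v.mem i)).Kept v.mem w.mem := hcbOK.cb_kept (hkept _ hcbOK.F2) i h.cur.lt
  have hsf := Codebook.SameFields.of_kept hstruct
  have hfresh := h.fresh
  refine ⟨?_, by rw [hcb, hsf.entries]⟩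
  exact
    { frame := hF
      cur := hC
      k1 := by
        rw [hcb]
        have hk := h.k1
        exact ⟨by rw [hsf.dimensions]; exact hk.dim_pos, by rw [hsf.dimensions]; exact hk.dim_le,
          by rw [hsf.entries]; exact hk.ent_nonneg, by rw [hsf.entries]; exact hk.ent_lt⟩
      sparse := by rw [hcb, hsf.sparse]; exact h.sparse
      cl0 := by rw [hcb, hsf.codeword_lengths]; exact h.cl0
      fresh := by
        rw [hcb]
        exact ⟨⟨⟨by rw [hsf.lookup_type]; exact hfresh.lookup_type, by rw [hsf.lookup_values]; exact hfresh.lookup_values,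
          by rw [hsf.multiplicands]; exact hfresh.multiplicands⟩, by rw [hsf.sorted_codewords]; exact hfresh.sorted_codewords,
          by rw [hsf.sorted_values]; exact hfresh.sorted_values⟩, by rw [hsf.codewords]; exact hfresh.codewords,
          by rw [hsf.sorted_entries]; exact hfresh.sorted_entries⟩
      r12 := by rw [hr12]; exact h.r12
      o_lt := h.o_lt
      ord := h.ord }

/-- What `In6.step` returns at the new state `w`: `Frame` (at `pc'`), CUR(i), and the clauses of `In6` about the struct `cb(i)` except
`codeword_lengths` (the one field segment C2 stores after the allocation). -/
structure Out6 (u₀ : State) (g : Ghost) (i : Nat) (A2 A3 Ai : Arena) (A' : Arena × List Obj) (pc' : Word) (sp o : Nat) (v w : State) :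
    Prop where
  frame : Frame u₀ g pc' A' w
  cur : Cur g i A2 A3 Ai A' w
  cb : g.cb w.mem i = g.cb v.mem i
  k1 : Codebook.K1 w.mem (g.cb w.mem i)
  sparse : Codebook.sparse w.mem (g.cb w.mem i) = sp
  fresh : Fresh7 w.mem (g.cb w.mem i)
  entries : Codebook.entries w.mem (g.cb w.mem i) = Codebook.entries v.mem (g.cb v.mem i)
  r12 : w.reg .r12 = addr o

/-- **`In6` over a step of segment C2 after the allocation** (the check call and the store of `c->codeword_lengths`; the ERRSTUB's `call error`):
the ghost arena stays; every window is an `OkWin0`, and of the struct `cb(i)` at most `[c + 8, c + 16)` is written. -/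
theorem In6.step {u₀ : State} {g : Ghost} {i : Nat} {A2 A3 Ai : Arena} {A' : Arena × List Obj} {pc pc' : Word} {sp o : Nat}
    {v w : State} {ws : List Span} (h : In6 u₀ g i A2 A3 Ai A' pc sp o v)
    (hs : Mem.SameExcept ws v.mem w.mem) (hun : ShadowUntouched v.mem w.mem)
    (hok : ∀ x, x ∈ ws → OkWin0 g (g.cb v.mem i) x)
    (hcl : ∀ x, x ∈ ws → x.hi ≤ g.cb v.mem i ∨ g.cb v.mem i + 2120 ≤ x.lo ∨ (g.cb v.mem i + 8 ≤ x.lo ∧ x.hi ≤ g.cb v.mem i + 16))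
    (hb : Bits (g.Blk A') g.len w.mem g.f) (hrip : w.rip = pc') (hrsp : w.reg .rsp = v.reg .rsp) (hcode : CodeOK u₀ w.mem)
    (hinv : abiInv w) (hr14 : w.reg .r14 = v.reg .r14) (hr12 : w.reg .r12 = v.reg .r12) :
    Out6 u₀ g i A2 A3 Ai A' pc' sp o v w := by
  have hfr' := Frame.step h.frame h.cur hs hun (fun x hx => (hok x hx).ok) hb hrip hrsp hcode hinv
  obtain ⟨hcur', hcb⟩ := Cur.step h.frame h.cur hs hun (fun x hx => (hok x hx).ok) hb hr14
  have hcwh := (MInv.of h.frame h.cur).c_where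
  obtain ⟨c, hc⟩ : ∃ c, g.cb v.mem i = c := ⟨_, rfl⟩
  rw [hc] at hcl hcwh
  have e1 : Mem.EqOn c (c + 8) v.mem w.mem := by
    apply hs.eqOn
    intro x hx
    have := hcl x hx
    omega
  have e2 : Mem.EqOn (c + 16) (c + 2120) v.mem w.mem := by
    apply hs.eqOn
    intro x hx
    have := hcl x hx
    omega
  have hk := h.k1
  have hf := h.fresh
  have hsp := h.sparse
  rw [hc] at hk hf hsp
  have hwr : c + 2120 ≤ 2 ^ 64 := by omega
  have edim : Codebook.dimensions w.mem c = Codebook.dimensions v.mem c := by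
    simp only [vacc, voff]
    exact e1.i32 _ (by omega) (by omega) (by omega)
  have eent : Codebook.entries w.mem c = Codebook.entries v.mem c := by
    simp only [vacc, voff]
    exact e1.i32 _ (by omega) (by omega) (by omega)
  refine
    { frame := hfr'
      cur := hcur'
      cb := by rw [hcb, hc]
      k1 := ?_
      sparse := ?_
      fresh := ?_
      entries := by rw [hcb, hc, eent]
      r12 := by rw [hr12]; exact h.r12 }
  · rw [hcb, hc]
    exact ⟨by rw [edim]; exact hk.dim_pos, by rw [edim]; exact hk.dim_le, by rw [eent]; exact hk.ent_nonneg,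
      by rw [eent]; exact hk.ent_lt⟩
  · rw [hcb, hc, ← hsp]
    simp only [vacc, voff]
    exact e2.u8 _ (by omega) (by omega) (by omega)
  · rw [hcb, hc]
    have f1 := hf.lookup_type
    have f2 := hf.lookup_values
    have f3 := hf.multiplicands
    have f4 := hf.sorted_codewords
    have f5 := hf.sorted_values
    have f6 := hf.codewords
    have f7 := hf.sorted_entries
    simp only [vacc, voff] at f1 f2 f3 f4 f5 f6 f7
    refine ⟨⟨⟨?_, ?_, ?_⟩, ?_, ?_⟩, ?_, ?_⟩
    · simp only [vacc, voff]
      rw [e2.u8 _ (by omega) (by omega) (by omega)]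
      exact f1
    · simp only [vacc, voff]
      rw [e2.u32 _ (by omega) (by omega) (by omega)]
      exact f2
    · simp only [vacc, voff]
      rw [e2.u64 _ (by omega) (by omega) (by omega)]
      exact f3
    · simp only [vacc, voff]
      rw [e2.u64 _ (by omega) (by omega) (by omega)]
      exact f4
    · simp only [vacc, voff]
      rw [e2.u64 _ (by omega) (by omega) (by omega)]
      exact f5
    · simp only [vacc, voff]
      rw [e2.u64 _ (by omega) (by omega) (by omega)]
      exact f6
    · simp only [vacc, voff]
      rw [e2.i32 _ (by omega) (by omega) (by omega)]
      exact f7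

/-- **The exit `AtC3`** (0x1144ee, `ordered ≠ 0`: the book is dense): `lengths = codeword_lengths = p`, the block allocated since the head of
the iteration. -/
theorem exitC3 {u₀ : State} {g : Ghost} {i : Nat} {A2 A3 Ai : Arena} {A : Arena × List Obj} {o p : Nat} {v w : State}
    (h : Out6 u₀ g i A2 A3 Ai A pc_C3 0 o v w) (hnt : A.1.temps = [])
    (hsince : Since Ai A.1 ⟨p, (Codebook.entries v.mem (g.cb v.mem i)).toNat⟩)
    (hcl : Codebook.codeword_lengths w.mem (g.cb w.mem i) = p) (hrbx : w.reg .rbx = addr p) : AtC3 u₀ g i w := by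
  refine ⟨A, A2, A3, Ai, ?_⟩
  exact
    { frame := h.frame
      cur := h.cur
      k1 := h.k1
      sparse0 := h.sparse
      rbx := by rw [hcl]; exact hrbx
      lengths := by rw [hcl, h.entries]; exact hsince
      noTemps := hnt
      fresh := h.fresh }

/-- **The exit `AtC4`** (0x1147c3, `ordered = 0`), first arrival at the head of loop 3786: `j = total = 0`, `rbx = lengths = p`; where the
array is (`LengthsAt`) is given. -/
theorem exitC4 {u₀ : State} {g : Ghost} {i : Nat} {A2 A3 Ai : Arena} {A : Arena × List Obj} {sp p : Nat} {v w : State}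
    (h : Out6 u₀ g i A2 A3 Ai A pc_C4 sp 0 v w) (hrbx : w.reg .rbx = addr p) (hrbp : w.reg .rbp = addr 0)
    (hplace : LengthsAt (Since Ai A.1) A w.mem (g.cb w.mem i) p) : AtC4 u₀ g i w := by
  refine ⟨A, p, 0, A2, A3, Ai, ?_⟩
  exact
    { frame := h.frame
      cur := h.cur
      k1 := h.k1
      r12 := h.r12
      j_le := h.k1.ent_nonneg
      rbp := hrbp
      rbx := hrbx
      lenL := fun j hj => absurd hj (Nat.not_lt_zero j)
      place := hplace
      fresh := h.fresh }

/-- **The exit `AtERR`** after the ERRSTUB(3) of line 3771 (`lengths = NULL`): SD.ERR from CUR(i) (`Cur.failed`), eax = 0. -/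
theorem exitERR {u₀ : State} {g : Ghost} {i : Nat} {A2 A3 Ai : Arena} {A : Arena × List Obj} {sp o : Nat} {v w : State}
    (h : Out6 u₀ g i A2 A3 Ai A pc_ERR sp o v w) (hax : (w.reg .rax).toNat % 2 ^ 32 = 0) : AtERR u₀ g w :=
  ⟨A, h.frame, h.cur.hand, Or.inl ⟨hax, h.cur.failed⟩⟩

/-- **Where `*f` is** (a stack object of stb_vorbis_open_memory, or an object of `A.2`): in the data space, and off the part of the stack below
the steady stack pointer `R`. -/
theorem obj_where5 {g : Ghost} {i : Nat} {A2 A3 Ai : Arena} {A : Arena × List Obj} {v : State} (h : Cur g i A2 A3 Ai A v)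
    (hsh : ShadowInv A.2 g.frames' g.R v.mem) (hoff : ∀ o, o ∈ A.2 → L.textHi ≤ o.base) :
    0x119d40 ≤ g.f ∧ g.f + 1808 ≤ 0xC00000 ∧ (g.R ≤ g.f ∨ g.f + 1808 ≤ 0x700000 ∨ 0x800000 ≤ g.f) := by
  have hl : LiveIn A.2 g.frames' g.f Off.sizeof.stb_vorbis := h.hand.obj.mono (sub_frames' g A)
  have hw := hl.where_ hsh hoff (by simp only [voff]; omega)
  simp only [voff] at hw
  exact hw

/-- **The precondition of `setup_malloc` / `setup_temp_malloc` at their call** (`ArenaPre`): the state `s` at the callee's entry has the memory of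
the cut point but for the pushed return address below `R`, `rsp = R − 8`, `rdi = f`. -/
theorem arena_pre5 {u₀ : State} {g : Ghost} {i : Nat} {A2 A3 Ai : Arena} {A : Arena × List Obj} {pc : Word} {v s : State}
    (hfr : Frame u₀ g pc A v) (hcur : Cur g i A2 A3 Ai A v) (hun : ShadowUntouched v.mem s.mem)
    (hmem : Mem.EqOn (g.f + 112) (g.f + 136) v.mem s.mem) (hrsp : (s.reg .rsp).toNat + 8 = g.R)
    (hrdi : (s.reg .rdi).toNat = g.f) : ArenaPre A.1 A.2 g.frames' s := by
  have hob := hcur.sd.bits.OB1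
  obtain ⟨hf1, hf2, _⟩ := obj_where5 hcur hfr.shadow hfr.offText
  refine ⟨⟨?_, hfr.offText⟩, ?_, ?_, hcur.hand.arenaText⟩
  · rw [hrsp]
    exact hfr.shadow.untouched hun
  · rw [hrdi]
    exact hcur.sd.env.live _ hob
  · rw [hrdi]
    apply hcur.sd.arena.frame (by simp only [voff]; omega)
    simp only [voff]
    exact hmem

/-- **Line 3769, the dense allocation** (`ret130` 0x1144b4: `esi = c->entries ; rdi = f ; call setup_malloc` → `cut99` 0x1144c2): both arms of the
allocator's contract; `In6` for the ghost arena after the call, `rax = 0` or the new block (allocated since the head of the iteration). -/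
theorem dense1 {Lay : Layout} (hLay : Lay.hi = 0x1000000) {μ : Microarch} (hμ : UserX.MicroOK μ) {u₀ : State}
    (hcode : HasCodeNat Lay u₀ Vorbis.L.start_decoder.entry Vorbis.Code.code_start_decoder.nat Vorbis.L.start_decoder.size)
    (h_malloc : ∀ (others : List Obj) (frames : List (Nat × FrameLayout)) (A : Arena),
      Calls Lay μ Vorbis.WayInv (Vorbis.conv u₀) Vorbis.L.setup_malloc.entry (Vorbis.Spec.setup_malloc.spec others frames A))
    (g : Ghost) (i : Nat) (v : State) (A2 A3 : Arena) (A : Arena × List Obj) (o : Nat)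
    (h5 : In5 u₀ g i A2 A3 A Vorbis.L.start_decoder.ret130 0 o v) :
    ReachVia Lay μ WayInv v (fun w => ∃ A' : Arena × List Obj, In6 u₀ g i A2 A3 A.1 A' Vorbis.L.start_decoder.cut99 0 o w ∧
      A'.1.temps = [] ∧ (w.reg .rax = 0 ∨
        Since A.1 A'.1 ⟨(w.reg .rax).toNat, (Codebook.entries w.mem (g.cb w.mem i)).toNat⟩)) := by
  have hfr := h5.frame
  have hcur := h5.cur
  have hh := hcur.hand
  have he := hfr.entry
  v_entry he
  simp only [depth] at he_room he_stack
  have hwhere := f_where hfr hh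
  have hRA : g.RA = (g.e.reg .rsp).toNat := rfl
  rw [hRA] at hwhere
  have w_rip : v.rip = Vorbis.L.start_decoder.ret130 := hfr.rip
  have hv_rsp : v.reg .rsp = g.e.reg .rsp - 1480 := by
    rw [hfr.rsp]
    unfold Ghost.R Ghost.RA steady
    have := slot_word (g.e.reg .rsp) 0 (by omega) (by omega)
    simpa using this
  obtain ⟨c, hcdef⟩ : ∃ c, g.cb v.mem i = c := ⟨_, rfl⟩
  have w_eq : Mem.EqOn Vorbis.L.textLo Vorbis.L.textHi u₀.mem v.mem := hfr.code
  have hdf : v.flags .df = false := (show abiInv _ from hfr.inv).1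
  have hmx : v.mxcsr &&& 0x1F80 = 0x1F80 := (show abiInv _ from hfr.inv).2
  have hsse := Vorbis.sseOK_of_abiInv hfr.inv
  have hfN : (UInt64.ofNat g.f).toNat = g.f := by u_omega
  have hcbok := hcur.ages.cbOK
  have hci := hcbok.cb_in i hcur.lt
  have hcbin := arena_inside hcur.sd.arena hcbok.F2
  have hcboff := hcur.sd.arena.blk_off_stack hcbok.F2
  have hAR1 := hcur.sd.arena.AR1
  have hout := hh.objOut
  have htext := hh.arenaText
  have hcb0 : g.cb v.mem i = c := hcdef
  unfold Ghost.cb at hcdef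
  rw [hcdef] at hci
  simp only [vblock, voff] at hci hcbin hcboff hout
  have htx : Vorbis.L.textHi = 0x119d40 := rfl
  rw [htx] at htext
  have hcw : 0x119d40 ≤ c ∧ c + 2120 ≤ 0xC00000 ∧ (c + 2120 ≤ 0x700000 ∨ 0x800000 ≤ c) ∧
      (g.f + 1808 ≤ c ∨ c + 2120 ≤ g.f) := by
    omega
  clear hci hcbin hcboff hAR1 hout htext
  have hcN : (UInt64.ofNat c).toNat = c := by u_omega
  have hv_r14 : v.reg .r14 = UInt64.ofNat c := by
    rw [hcur.r14, hcb0]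
    rfl
  have hv_f : v.mem.readLE (g.e.reg .rsp - 1456) 8 = g.f := by
    have := hcur.slot_f
    unfold Mem.u64 Ghost.R Ghost.RA steady at this
    rw [slot_word (g.e.reg .rsp) 0x18 (by omega) (by omega)] at this
    exact this
  have hm := h_malloc A.2 g.frames' A.1
  u_walk hcode [hμ.vendor] until [Vorbis.L.start_decoder.cut99] span [Vorbis.L.textLo, Vorbis.L.textHi] side (v_side)
  case call_inv => v_inv
  case pre_1144bd =>
    -- the precondition of setup_malloc(f, c->entries) at 0x1144bd
    have hun : ShadowUntouched v.mem s_1144bd.mem := by v_untouched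
    apply arena_pre5 hfr hcur hun
    · rw [w_mem]
      apply Mem.EqOn.writeLE
      · u_omega
      · u_omega
    · rw [w_rsp]
      unfold Ghost.R Ghost.RA steady
      u_omega
    · rw [w_rdi]
      exact hfN
  -- 0x1144c2 (`cut99`): setup_malloc(f, c->entries) returned
  obtain ⟨E, hE⟩ : ∃ E, v.mem.readLE (UInt64.ofNat c + 4) 4 = E := ⟨_, rfl⟩
  have hElt : E < 2 ^ 32 := by
    rw [← hE]
    exact Mem.readLE_lt' _ _ 4
  have e4 : addr (c + 4) = UInt64.ofNat c + 4 := by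
    unfold addr
    rw [UInt64.ofNat_add]
    rfl
  have hent : Codebook.entries v.mem c = sint32 E := by
    simp only [vacc, voff]
    unfold Mem.i32 Mem.u32
    rw [e4, hE]
  have k1 := h5.k1
  rw [hcb0] at k1
  have hEn : (Codebook.entries v.mem c).toNat = E := by
    have h1 := sint32_cases E
    have h2 := k1.ent_nonneg
    have h3 := k1.ent_lt
    omega
  have ersi : (s_1144bd.reg .rsi).toNat % 2 ^ 32 = E := by
    rw [w_rsi_1144bd, hE, Vorbis.toNat_ofBV32, BitVec.toNat_ofNat]
    omega
  simp only [X86.User.Spec.footprint, vspec] at w_same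
  have e_sp : (s_1144bd.reg .rsp).toNat + 8 = g.R := by
    rw [w_rsp_1144bd]
    unfold Ghost.R Ghost.RA steady
    u_omega
  have e_a : (g.e.reg .rsp - 1488).toNat + 8 = g.R := by
    unfold Ghost.R Ghost.RA steady
    u_omega
  have e_rdi : (s_1144bd.reg .rdi).toNat = g.f := by
    rw [w_rdi_1144bd]
    exact hfN
  have hrsp' : s_1144bdr.reg .rsp = v.reg .rsp := by
    rw [w_rsp, hv_rsp]
  by_cases hfit : A.1.Fits ((s_1144bd.reg .rsi).toNat % 2 ^ 32)
  · -- the request fits: the ghost arena grows by the block of `codeword_lengths`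
    obtain ⟨r1, r2, r3, r4, r5⟩ := Cur.alloc_call hfr hcur w_mem_1144bd e_a e_sp e_rdi w_same w_post hfit w_rip hrsp'
      (Vorbis.conv_code_eqOn w_code) w_inv (w_kept.get .r14 rfl)
    obtain ⟨h6, eent⟩ := In6.build h5 r1 r2 r3 r4 (w_kept.get .r12 rfl)
    refine ReachVia.done ⟨_, h6, h5.noTemps, Or.inr ?_⟩
    have hsince := hcur.sd.arena.since_pushSetup ((s_1144bd.reg .rsi).toNat % 2 ^ 32)
    rw [r5, eent, hcb0, hEn, ← ersi, Nat.add_assoc]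
    exact hsince
  · -- the request does not fit: rax = 0, the same ghost
    obtain ⟨r1, r2, r3, r4, r5⟩ := Cur.alloc_fail_any hfr hcur w_mem_1144bd e_a e_sp e_rdi w_same w_post hfit w_rip hrsp'
      (Vorbis.conv_code_eqOn w_code) w_inv (w_kept.get .r14 rfl)
    obtain ⟨h6, _⟩ := In6.build h5 r1 r2 r3 r4 (w_kept.get .r12 rfl)
    exact ReachVia.done ⟨A, h6, h5.noTemps, Or.inl r5⟩

/-- **Line 3769, second half, and lines 3771 – 3773 on the dense path** (`cut99` 0x1144c2: `rbx = rax` ; check store8 `c + 8` ;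
`c->codeword_lengths = rbx` ; `test rbx, rbx ; je` ERRSTUB(3) → `AtERR` ; `test r12d, r12d ; jne` → `AtC3` ; `ebp = 0 ; jmp` → `AtC4`). -/
theorem dense2 {Lay : Layout} (hLay : Lay.hi = 0x1000000) {μ : Microarch} (hμ : UserX.MicroOK μ) {u₀ : State}
    (hcode : HasCodeNat Lay u₀ Vorbis.L.start_decoder.entry Vorbis.Code.code_start_decoder.nat Vorbis.L.start_decoder.size)
    (hst8 : Asan.SmallCheck Lay μ Vorbis.WayInv (Vorbis.CodeOK u₀) [.rax, .rcx, .rdx] 8 Vorbis.L.__asan_store8_noabort.entry)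
    (h_error : ∀ (others : List Obj) (frames : List (Nat × FrameLayout)),
      Calls Lay μ Vorbis.WayInv (Vorbis.conv u₀) Vorbis.L.error.entry (Vorbis.Spec.error.spec others frames))
    (g : Ghost) (i : Nat) (v : State) (A2 A3 Ai : Arena) (A : Arena × List Obj) (o : Nat)
    (h6 : In6 u₀ g i A2 A3 Ai A Vorbis.L.start_decoder.cut99 0 o v) (hnt : A.1.temps = [])
    (hal : v.reg .rax = 0 ∨ Since Ai A.1 ⟨(v.reg .rax).toNat, (Codebook.entries v.mem (g.cb v.mem i)).toNat⟩) :
    ReachVia Lay μ WayInv v (fun w => AtC3 u₀ g i w ∨ AtC4 u₀ g i w ∨ AtC16 u₀ g w ∨ AtERR u₀ g w) := by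
  have hfr := h6.frame
  have hcur := h6.cur
  have hh := hcur.hand
  have he := hfr.entry
  v_entry he
  simp only [depth] at he_room he_stack
  have hpos : Pos g A := Pos.of hfr hcur
  have hwhere := f_where hfr hh
  have hRA : g.RA = (g.e.reg .rsp).toNat := rfl
  rw [hRA] at hwhere
  have w_rip : v.rip = Vorbis.L.start_decoder.cut99 := hfr.rip
  have hv_rsp : v.reg .rsp = g.e.reg .rsp - 1480 := by
    rw [hfr.rsp]
    unfold Ghost.R Ghost.RA steady
    have := slot_word (g.e.reg .rsp) 0 (by omega) (by omega)
    simpa using this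
  obtain ⟨c, hcb0⟩ : ∃ c, g.cb v.mem i = c := ⟨_, rfl⟩
  have w_eq : Mem.EqOn Vorbis.L.textLo Vorbis.L.textHi u₀.mem v.mem := hfr.code
  have hdf : v.flags .df = false := (show abiInv _ from hfr.inv).1
  have hmx : v.mxcsr &&& 0x1F80 = 0x1F80 := (show abiInv _ from hfr.inv).2
  have hsse := Vorbis.sseOK_of_abiInv hfr.inv
  have hfN : (UInt64.ofNat g.f).toNat = g.f := by u_omega
  have hcwh := (MInv.of hfr hcur).c_where
  have htext := hh.arenaText
  have htx : Vorbis.L.textHi = 0x119d40 := rfl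
  have hout := hpos.objOut
  rw [hcb0] at hcwh
  rw [htx] at htext
  have hcw : 0x119d40 ≤ c ∧ c + 2120 ≤ 0xC00000 ∧ (c + 2120 ≤ 0x700000 ∨ 0x800000 ≤ c) ∧
      (g.f + 1808 ≤ c ∨ c + 2120 ≤ g.f) := by
    omega
  have hcar : A.1.B ≤ c ∧ c + 2120 ≤ A.1.B + A.1.L := hcwh.1
  clear hcwh htext hout
  have hcN : (UInt64.ofNat c).toNat = c := by u_omega
  have hv_r14 : v.reg .r14 = UInt64.ofNat c := by
    rw [hcur.r14, hcb0]
    rfl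
  have hv_r12 : v.reg .r12 = UInt64.ofNat o := h6.r12
  have hv_f : v.mem.readLE (g.e.reg .rsp - 1456) 8 = g.f := by
    have := hcur.slot_f
    unfold Mem.u64 Ghost.R Ghost.RA steady at this
    rw [slot_word (g.e.reg .rsp) 0x18 (by omega) (by omega)] at this
    exact this
  have herr := h_error A.2 g.frames'
  have hl : LiveIn A.2 g.frames' g.f 1808 := hh.obj.mono (sub_frames' g A)
  have hlive : LiveBytes A.2 g.frames' c 2120 := by
    have hcbok := hcur.ages.cbOK
    have hbl := hcur.sd.env.live _ (up g A _ (hcbok.F2.mono hcur.ages.exti))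
    have hci' := hcbok.cb_in i hcur.lt
    unfold Ghost.cb at hcb0
    rw [hcb0] at hci'
    simp only [vblock, voff] at hci'
    exact LiveBytes.of_block hbl (by simp only []; omega) (by simp only [voff]; omega)
  obtain ⟨p, hp⟩ : ∃ p, (v.reg .rax).toNat = p := ⟨_, rfl⟩
  have hv_rax : v.reg .rax = UInt64.ofNat p := by
    rw [← hp]
    exact (UInt64.ofNat_toNat).symm
  have hpN : (UInt64.ofNat p).toNat = p := by
    rw [← hv_rax]
    exact hp
  u_walk hcode [hμ.vendor] until [Vorbis.L.start_decoder.cut4, Vorbis.L.start_decoder.cut101, Vorbis.L.start_decoder.cut122] span [Vorbis.L.textLo, Vorbis.L.textHi] side (v_side)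
  case check_1144c9 =>
    -- 0x1144c9 check store8 c+8 (line 3769 `c->codeword_lengths`): inside the codebooks block
    have hun : ShadowUntouched v.mem s_1144c9.mem := by v_untouched
    exact hlive.accSmall hfr.shadow hun _ 8 (by decide) (by u_omega) (by u_omega)
  case call_inv => v_inv
  case pre_1144e4 =>
    -- the precondition of error(f, VORBIS_outofmem) at 0x1144e4
    have hun : ShadowUntouched v.mem s_1144e4.mem := by v_untouched
    have hrdi : (s_1144e4.reg .rdi).toNat = g.f := by
      rw [w_rdi]
      exact hfN
    refine ⟨shadowPre_call hfr ?_ hun, ?_⟩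
    · rw [w_rsp]
      unfold Ghost.R Ghost.RA steady
      u_omega
    · rw [hrdi]
      exact hl
  · -- after error returned (0x1144e9 `jmp 113b22`): the exit AtERR with eax = 0 (line 3771, `lengths = NULL`)
    obtain ⟨hrax, hunp, _⟩ := w_post
    v_after_call w_rsp_1144e4 w_mem_1144e4
    simp only [w_rdi_1144e4, hfN, voff] at w_same
    have hs0 : Mem.SameExcept [⟨(g.e.reg .rsp).toNat - 1888, (g.e.reg .rsp).toNat - 1480⟩,
        ⟨g.f + 140, g.f + 144⟩, ⟨c + 8, c + 16⟩] v.mem s_1144e4r.mem := by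
      u_same
    have hun0 : ShadowUntouched v.mem s_1144e4r.mem := by v_untouched
    have w_rax : s_1144e4r.reg .rax = 0 := hrax
    u_walk hcode [hμ.vendor] until [Vorbis.L.start_decoder.cut4] span [Vorbis.L.textLo, Vorbis.L.textHi] side (v_side)
    have hs : Mem.SameExcept [⟨(g.e.reg .rsp).toNat - 1888, (g.e.reg .rsp).toNat - 1480⟩,
        ⟨g.f + 140, g.f + 144⟩, ⟨c + 8, c + 16⟩] v.mem s_1144e9.mem := by
      rw [w_mem]
      exact hs0
    have hun : ShadowUntouched v.mem s_1144e9.mem := by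
      rw [w_mem]
      exact hun0
    have hrsp : s_1144e9.reg .rsp = v.reg .rsp := by
      rw [w_rsp, hv_rsp]
    have hinv : abiInv s_1144e9 := by v_inv
    have hreq := hpos.r_eq
    rw [hRA] at hreq
    have hb : Bits (g.Blk A) g.len s_1144e9.mem g.f := by
      apply bits_kept hpos hcur.sd.bits hs
      intro x hx
      simp only [List.mem_cons, List.mem_nil_iff, or_false] at hx
      rcases hx with rfl | rfl | rfl <;> simp only [] <;> omega
    rw [← hcb0] at hs
    have hout := In6.step (pc' := pc_ERR) h6 hs hun (by
      intro x hx
      rw [hcb0]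
      simp only [List.mem_cons, List.mem_nil_iff, or_false] at hx
      unfold OkWin0
      rcases hx with rfl | rfl | rfl <;> simp only [] <;> omega) (by
      intro x hx
      rw [hcb0]
      simp only [List.mem_cons, List.mem_nil_iff, or_false] at hx
      rcases hx with rfl | rfl | rfl <;> simp only [] <;> omega) hb w_rip hrsp w_eq hinv (w_kept .r14 rfl) (w_kept .r12 rfl)
    refine ReachVia.done (Or.inr (Or.inr (Or.inr (exitERR hout ?_))))
    rw [w_rax]
    rfl
  · -- 0x1144ee (`cut101`), `ordered ≠ 0`: the exit AtC3
    have hs : Mem.SameExcept [⟨(g.e.reg .rsp).toNat - 1888, (g.e.reg .rsp).toNat - 1480⟩, ⟨c + 8, c + 16⟩]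
        v.mem s_114407.mem := by
      u_same
    have hun : ShadowUntouched v.mem s_114407.mem := by v_untouched
    have hrsp : s_114407.reg .rsp = v.reg .rsp := by
      rw [w_rsp, hv_rsp]
    have hinv : abiInv s_114407 := by v_inv
    have hreq := hpos.r_eq
    rw [hRA] at hreq
    have hb : Bits (g.Blk A) g.len s_114407.mem g.f := by
      apply bits_kept hpos hcur.sd.bits hs
      intro x hx
      simp only [List.mem_cons, List.mem_nil_iff, or_false] at hx
      rcases hx with rfl | rfl <;> simp only [] <;> omega
    rw [← hcb0] at hs
    have hout := In6.step (pc' := pc_C3) h6 hs hun (by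
      intro x hx
      rw [hcb0]
      simp only [List.mem_cons, List.mem_nil_iff, or_false] at hx
      unfold OkWin0
      rcases hx with rfl | rfl <;> simp only [] <;> omega) (by
      intro x hx
      rw [hcb0]
      simp only [List.mem_cons, List.mem_nil_iff, or_false] at hx
      rcases hx with rfl | rfl <;> simp only [] <;> omega) hb w_rip hrsp w_eq hinv (w_kept .r14 rfl) (w_kept .r12 rfl)
    have hpne : v.reg .rax ≠ 0 := by
      intro h0
      rw [hv_rax] at h0
      apply hbr_1143fe
      rw [h0]
      rfl
    have hsince := hal.resolve_left hpne
    rw [hp] at hsince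
    have hcl : Codebook.codeword_lengths s_114407.mem (g.cb s_114407.mem i) = p := by
      rw [hout.cb, hcb0]
      simp only [vacc, voff]
      unfold Mem.u64
      have e8 : addr (c + 8) = UInt64.ofNat c + 8 := by
        unfold addr
        rw [UInt64.ofNat_add]
        rfl
      rw [e8, w_mem, hpN]
      u_read
    refine ReachVia.done (Or.inl (exitC3 hout hnt hsince hcl ?_))
    rw [w_rbx]
    rfl
  · -- 0x1147c3 (`cut122`), `ordered = 0`: the exit AtC4 with j = total = 0, the dense array
    have hs : Mem.SameExcept [⟨(g.e.reg .rsp).toNat - 1888, (g.e.reg .rsp).toNat - 1480⟩, ⟨c + 8, c + 16⟩]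
        v.mem s_114410.mem := by
      u_same
    have hun : ShadowUntouched v.mem s_114410.mem := by v_untouched
    have hrsp : s_114410.reg .rsp = v.reg .rsp := by
      rw [w_rsp, hv_rsp]
    have hinv : abiInv s_114410 := by v_inv
    have hreq := hpos.r_eq
    rw [hRA] at hreq
    have hb : Bits (g.Blk A) g.len s_114410.mem g.f := by
      apply bits_kept hpos hcur.sd.bits hs
      intro x hx
      simp only [List.mem_cons, List.mem_nil_iff, or_false] at hx
      rcases hx with rfl | rfl <;> simp only [] <;> omega
    rw [← hcb0] at hs
    have hout := In6.step (pc' := pc_C4) h6 hs hun (by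
      intro x hx
      rw [hcb0]
      simp only [List.mem_cons, List.mem_nil_iff, or_false] at hx
      unfold OkWin0
      rcases hx with rfl | rfl <;> simp only [] <;> omega) (by
      intro x hx
      rw [hcb0]
      simp only [List.mem_cons, List.mem_nil_iff, or_false] at hx
      rcases hx with rfl | rfl <;> simp only [] <;> omega) hb w_rip hrsp w_eq hinv (w_kept .r14 rfl) (w_kept .r12 rfl)
    have hpne : v.reg .rax ≠ 0 := by
      intro h0
      rw [hv_rax] at h0
      apply hbr_1143fe
      rw [h0]
      rfl
    have hsince := hal.resolve_left hpne
    rw [hp] at hsince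
    have hcl : Codebook.codeword_lengths s_114410.mem (g.cb s_114410.mem i) = p := by
      rw [hout.cb, hcb0]
      simp only [vacc, voff]
      unfold Mem.u64
      have e8 : addr (c + 8) = UInt64.ofNat c + 8 := by
        unfold addr
        rw [UInt64.ofNat_add]
        rfl
      rw [e8, w_mem, hpN]
      u_read
    have ho0 : o = 0 := by
      have ho := h6.o_lt
      have e32 : (Word.part Width.w32 (UInt64.ofNat o)).toNat = o := by
        rw [Vorbis.toNat_part32]
        have : (UInt64.ofNat o).toNat = o := by u_omega
        omega
      omega
    subst ho0
    refine ReachVia.done (Or.inr (Or.inl (exitC4 (p := p) hout ?_ ?_ ?_)))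
    · rw [w_rbx]
      rfl
    · rw [w_rbp]
      rfl
    · exact
        { sparse_01 := Or.inl hout.sparse
          sparse_temp := fun h1 => absurd (hout.sparse.symm.trans h1) (by decide)
          sparse_null := fun h1 => absurd (hout.sparse.symm.trans h1) (by decide)
          dense_block := fun _ => by rw [hout.entries]; exact hsince
          dense_eq := fun _ => hcl.symm
          dense_temps := fun _ => hnt }

/-- **A WHOLE `call setup_temp_malloc` THAT SUCCEEDS, in the walker's terms** (the analogue of `Cur.alloc_call` for the temp allocator): `v` = the
cut point, `s` = the state at the callee's entry (`hmem`: the pushed return address), `sr` = the returned state; `hs` = `w_same` after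
`simp only [X86.User.Spec.footprint, vspec]`. Gives `Frame` and CUR(i) at `sr` for the ghost `(A.1.pushTemp n, A.1.newTempObj n :: A.2)`, `cb(i)`
unmoved, every setup block kept, rax = the new temp block. -/
theorem temp_call_fits {u₀ : State} {g : Ghost} {pc pc' : Word} {i : Nat} {A2 A3 Ai : Arena} {A : Arena × List Obj}
    {v s sr : State} {a : Word} {x : Nat} (h : Frame u₀ g pc A v) (hc : Cur g i A2 A3 Ai A v)
    (hmem : s.mem = v.mem.writeLE a 8 x) (ha : a.toNat + 8 = g.R) (hsp : (s.reg .rsp).toNat + 8 = g.R)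
    (hrdi : (s.reg .rdi).toNat = g.f)
    (hs : Mem.SameExcept [⟨(s.reg .rsp).toNat - 80, (s.reg .rsp).toNat⟩,
      ⟨(s.reg .rdi).toNat + 132, (s.reg .rdi).toNat + 136⟩,
      shadowSpan (A.1.B + (A.1.T - (r8 ((s.reg .rsi).toNat % 2 ^ 32) + 32)))
        (A.1.B + (A.1.T - (r8 ((s.reg .rsi).toNat % 2 ^ 32) + 32)) + (s.reg .rsi).toNat % 2 ^ 32)] s.mem sr.mem)
    (hpost : (setup_temp_malloc.spec A.2 g.frames' A.1).post s sr) (hfit : A.1.Fits ((s.reg .rsi).toNat % 2 ^ 32))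
    (hrip : sr.rip = pc') (hrsp : sr.reg .rsp = v.reg .rsp) (hcode : CodeOK u₀ sr.mem) (hinv : abiInv sr)
    (hr14 : sr.reg .r14 = v.reg .r14) :
    Frame u₀ g pc' (A.1.pushTemp ((s.reg .rsi).toNat % 2 ^ 32), A.1.newTempObj ((s.reg .rsi).toNat % 2 ^ 32) :: A.2) sr ∧
      Cur g i A2 A3 Ai (A.1.pushTemp ((s.reg .rsi).toNat % 2 ^ 32), A.1.newTempObj ((s.reg .rsi).toNat % 2 ^ 32) :: A.2) sr ∧
      g.cb sr.mem i = g.cb v.mem i ∧ AllKept A.1.Blk v.mem sr.mem ∧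
      (sr.reg .rax).toNat = A.1.B + (A.1.T - (r8 ((s.reg .rsi).toNat % 2 ^ 32) + 32)) := by
  obtain ⟨hrax, ha', hsh'⟩ := hpost.1 hfit
  rw [hrdi] at ha'
  rw [hsp] at hsh'
  rw [hrdi] at hs
  generalize (s.reg .rsi).toNat % 2 ^ 32 = n at *
  generalize (s.reg .rsp).toNat = sp at *
  have hpos := Pos.of h hc
  have p1 := hpos.r_eq
  have p2 := hpos.ra_hi
  have p3 := hpos.ra_lo
  have h2 := hc.sd.arena.AR2
  have hl := le_r8 n
  unfold Arena.Fits at hfit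
  have hext := A.1.extends_pushTemp n
  have hand' : g.Hand (A.1.pushTemp n, A.1.newTempObj n :: A.2) :=
    HandOK.mono hc.hand hext (fun o ho => List.mem_cons_of_mem _ ho)
  have hx : BlkLive (listBlk g.extra) (g.Live (A.1.pushTemp n, A.1.newTempObj n :: A.2)) := by
    have hl0 : BlkLive (listBlk g.extra) (g.Live A) := hc.sd.env.live.sub (fun B hB => runBlk_extra hB)
    refine hl0.mono (fun y hy => ?_)
    obtain ⟨o, ho, hb⟩ := hy
    refine ⟨o, ?_, hb⟩
    rcases List.mem_append.mp ho with hst | hoth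
    · exact List.mem_append_left _ hst
    · exact List.mem_append_right _ (List.mem_cons_of_mem _ hoth)
  have hoff' : ∀ o, o ∈ A.1.newTempObj n :: A.2 → L.textHi ≤ o.base := by
    intro o ho
    rcases List.mem_cons.mp ho with rfl | hold
    · have ht := hc.hand.arenaText
      show L.textHi ≤ A.1.B + (A.1.T - (r8 n + 32))
      omega
    · exact h.offText o hold
  have hall : Mem.SameExcept [⟨g.R - 88, g.R⟩, ⟨g.f + 132, g.f + 136⟩,
      shadowSpan (A.1.B + (A.1.T - (r8 n + 32))) (A.1.B + (A.1.T - (r8 n + 32)) + n)] v.mem sr.mem := by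
    refine Mem.SameExcept.trans (ν := s.mem) ?_ ?_
    · rw [hmem]
      apply Mem.SameExcept.writeLE
      · omega
      · refine ⟨_, List.mem_cons_self, ?_, ?_⟩
        · simp only []
          omega
        · simp only []
          omega
    · apply hs.mono
      intro w hw b h1 h2
      simp only [List.mem_cons, List.mem_nil_iff, or_false] at hw
      rcases hw with rfl | rfl | rfl
      · simp only [] at h1 h2
        exact ⟨_, List.mem_cons_self, by simp only []; omega, by simp only []; omega⟩
      · exact ⟨_, List.mem_cons_of_mem _ List.mem_cons_self, h1, h2⟩
      · exact ⟨_, List.mem_cons_of_mem _ (List.mem_cons_of_mem _ List.mem_cons_self), h1, h2⟩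
  have hok : ∀ w, w ∈ [(⟨g.R - 88, g.R⟩ : Span), ⟨g.f + 132, g.f + 136⟩,
      shadowSpan (A.1.B + (A.1.T - (r8 n + 32))) (A.1.B + (A.1.T - (r8 n + 32)) + n)] → AllocWin g A w := by
    intro w hw
    simp only [List.mem_cons, List.mem_nil_iff, or_false] at hw
    unfold AllocWin
    rcases hw with rfl | rfl | rfl
    · left
      simp only []
      omega
    · right
      right
      left
      simp only []
      omega
    · right
      right
      right
      simp only [shadowSpan]
      omega
  obtain ⟨r1, r2, r3, r4⟩ := Cur.free (A' := (A.1.pushTemp n, A.1.newTempObj n :: A.2)) h hc hall hok hext ha' hsh' hand' hx hoff'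
    hrip hrsp hcode hinv hr14
  exact ⟨r1, r2, r3, r4, hrax⟩

/-- **A WHOLE `call setup_temp_malloc` THAT FAILS** (the analogue of `Cur.alloc_fail_any`): rax = 0, the same ghost; the failure clause of the
callee's post carries the footprint of the failed call (its stack window). -/
theorem temp_call_fail {u₀ : State} {g : Ghost} {pc pc' : Word} {i : Nat} {A2 A3 Ai : Arena} {A : Arena × List Obj}
    {v s sr : State} {a : Word} {x : Nat} (h : Frame u₀ g pc A v) (hc : Cur g i A2 A3 Ai A v)
    (hmem : s.mem = v.mem.writeLE a 8 x) (ha : a.toNat + 8 = g.R) (hsp : (s.reg .rsp).toNat + 8 = g.R)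
    (hrdi : (s.reg .rdi).toNat = g.f)
    (hpost : (setup_temp_malloc.spec A.2 g.frames' A.1).post s sr) (hfit : ¬ A.1.Fits ((s.reg .rsi).toNat % 2 ^ 32))
    (hrip : sr.rip = pc') (hrsp : sr.reg .rsp = v.reg .rsp) (hcode : CodeOK u₀ sr.mem) (hinv : abiInv sr)
    (hr14 : sr.reg .r14 = v.reg .r14) :
    Frame u₀ g pc' A sr ∧ Cur g i A2 A3 Ai A sr ∧ g.cb sr.mem i = g.cb v.mem i ∧ AllKept A.1.Blk v.mem sr.mem ∧
      sr.reg .rax = 0 := by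
  obtain ⟨hrax, ha', hun, hfailSame⟩ := hpost.2 hfit
  rw [hrdi] at ha'
  have hpos := Pos.of h hc
  have p1 := hpos.r_eq
  have p2 := hpos.ra_hi
  have p3 := hpos.ra_lo
  have hun0 : ShadowUntouched v.mem s.mem := by
    rw [hmem]
    exact Mem.eqOn_writeLE v.mem a 8 x 0xC00000 0x200000 (by omega) (by omega)
  have hunAll : ShadowUntouched v.mem sr.mem := Mem.EqOn.trans hun0 hun
  have hsh' : ShadowInv A.2 g.frames' g.R sr.mem := h.shadow.untouched hunAll
  have hx : BlkLive (listBlk g.extra) (g.Live A) := hc.sd.env.live.sub (fun B hB => runBlk_extra hB)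
  have hall : Mem.SameExcept [⟨g.R - 88, g.R⟩] v.mem sr.mem := by
    refine Mem.SameExcept.trans (ν := s.mem) ?_ ?_
    · rw [hmem]
      apply Mem.SameExcept.writeLE
      · omega
      · refine ⟨_, List.mem_cons_self, ?_, ?_⟩
        · simp only []
          omega
        · simp only []
          omega
    · apply hfailSame.mono
      intro w hw b h1 h2
      simp only [List.mem_cons, List.mem_nil_iff, or_false] at hw
      subst hw
      simp only [] at h1 h2
      exact ⟨_, List.mem_cons_self, by simp only []; omega, by simp only []; omega⟩
  have hok : ∀ w, w ∈ [(⟨g.R - 88, g.R⟩ : Span)] → AllocWin g A w := by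
    intro w hw
    simp only [List.mem_cons, List.mem_nil_iff, or_false] at hw
    unfold AllocWin
    subst hw
    left
    simp only []
    omega
  obtain ⟨r1, r2, r3, r4⟩ := Cur.free h hc hall hok (Arena.Extends.refl _) ha' hsh' hc.hand hx h.offText hrip hrsp hcode
    hinv hr14
  exact ⟨r1, r2, r3, r4, hrax⟩

/-- **Line 3767, the sparse allocation** (`ret121` 0x1143ea: `esi = c->entries ; rdi = f ; call setup_temp_malloc` → `cut91` 0x1143f8): both arms of
the allocator's contract; `In6` for the ghost arena after the call, `rax = 0` or the new temp block P1 = (rax, E), the only one. -/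
theorem sparse1 {Lay : Layout} (hLay : Lay.hi = 0x1000000) {μ : Microarch} (hμ : UserX.MicroOK μ) {u₀ : State}
    (hcode : HasCodeNat Lay u₀ Vorbis.L.start_decoder.entry Vorbis.Code.code_start_decoder.nat Vorbis.L.start_decoder.size)
    (h_tmalloc : ∀ (others : List Obj) (frames : List (Nat × FrameLayout)) (A : Arena),
      Calls Lay μ Vorbis.WayInv (Vorbis.conv u₀) Vorbis.L.setup_temp_malloc.entry (Vorbis.Spec.setup_temp_malloc.spec others frames A))
    (g : Ghost) (i : Nat) (v : State) (A2 A3 : Arena) (A : Arena × List Obj) (o : Nat)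
    (h5 : In5 u₀ g i A2 A3 A Vorbis.L.start_decoder.ret121 1 o v) :
    ReachVia Lay μ WayInv v (fun w => ∃ A' : Arena × List Obj, In6 u₀ g i A2 A3 A.1 A' Vorbis.L.start_decoder.cut91 1 o w ∧
      (w.reg .rax = 0 ∨
        TempsAre A'.1 [((w.reg .rax).toNat, (Codebook.entries w.mem (g.cb w.mem i)).toNat)])) := by
  have hfr := h5.frame
  have hcur := h5.cur
  have hh := hcur.hand
  have he := hfr.entry
  v_entry he
  simp only [depth] at he_room he_stack
  have hwhere := f_where hfr hh
  have hRA : g.RA = (g.e.reg .rsp).toNat := rfl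
  rw [hRA] at hwhere
  have w_rip : v.rip = Vorbis.L.start_decoder.ret121 := hfr.rip
  have hv_rsp : v.reg .rsp = g.e.reg .rsp - 1480 := by
    rw [hfr.rsp]
    unfold Ghost.R Ghost.RA steady
    have := slot_word (g.e.reg .rsp) 0 (by omega) (by omega)
    simpa using this
  obtain ⟨c, hcdef⟩ : ∃ c, g.cb v.mem i = c := ⟨_, rfl⟩
  have w_eq : Mem.EqOn Vorbis.L.textLo Vorbis.L.textHi u₀.mem v.mem := hfr.code
  have hdf : v.flags .df = false := (show abiInv _ from hfr.inv).1
  have hmx : v.mxcsr &&& 0x1F80 = 0x1F80 := (show abiInv _ from hfr.inv).2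
  have hsse := Vorbis.sseOK_of_abiInv hfr.inv
  have hfN : (UInt64.ofNat g.f).toNat = g.f := by u_omega
  have hcbok := hcur.ages.cbOK
  have hci := hcbok.cb_in i hcur.lt
  have hcbin := arena_inside hcur.sd.arena hcbok.F2
  have hcboff := hcur.sd.arena.blk_off_stack hcbok.F2
  have hAR1 := hcur.sd.arena.AR1
  have hout := hh.objOut
  have htext := hh.arenaText
  have hcb0 : g.cb v.mem i = c := hcdef
  unfold Ghost.cb at hcdef
  rw [hcdef] at hci
  simp only [vblock, voff] at hci hcbin hcboff hout
  have htx : Vorbis.L.textHi = 0x119d40 := rfl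
  rw [htx] at htext
  have hcw : 0x119d40 ≤ c ∧ c + 2120 ≤ 0xC00000 ∧ (c + 2120 ≤ 0x700000 ∨ 0x800000 ≤ c) ∧
      (g.f + 1808 ≤ c ∨ c + 2120 ≤ g.f) := by
    omega
  clear hci hcbin hcboff hAR1 hout htext
  have hcN : (UInt64.ofNat c).toNat = c := by u_omega
  have hv_r14 : v.reg .r14 = UInt64.ofNat c := by
    rw [hcur.r14, hcb0]
    rfl
  have hv_f : v.mem.readLE (g.e.reg .rsp - 1456) 8 = g.f := by
    have := hcur.slot_f
    unfold Mem.u64 Ghost.R Ghost.RA steady at this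
    rw [slot_word (g.e.reg .rsp) 0x18 (by omega) (by omega)] at this
    exact this
  have hm := h_tmalloc A.2 g.frames' A.1
  u_walk hcode [hμ.vendor] until [Vorbis.L.start_decoder.cut91] span [Vorbis.L.textLo, Vorbis.L.textHi] side (v_side)
  case call_inv => v_inv
  case pre_1143f3 =>
    -- the precondition of setup_temp_malloc(f, c->entries) at 0x1143f3
    have hun : ShadowUntouched v.mem s_1143f3.mem := by v_untouched
    apply arena_pre5 hfr hcur hun
    · rw [w_mem]
      apply Mem.EqOn.writeLE
      · u_omega
      · u_omega
    · rw [w_rsp]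
      unfold Ghost.R Ghost.RA steady
      u_omega
    · rw [w_rdi]
      exact hfN
  -- 0x1143f8 (`cut91`): setup_temp_malloc(f, c->entries) returned
  obtain ⟨E, hE⟩ : ∃ E, v.mem.readLE (UInt64.ofNat c + 4) 4 = E := ⟨_, rfl⟩
  have hElt : E < 2 ^ 32 := by
    rw [← hE]
    exact Mem.readLE_lt' _ _ 4
  have e4 : addr (c + 4) = UInt64.ofNat c + 4 := by
    unfold addr
    rw [UInt64.ofNat_add]
    rfl
  have hent : Codebook.entries v.mem c = sint32 E := by
    simp only [vacc, voff]
    unfold Mem.i32 Mem.u32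
    rw [e4, hE]
  have k1 := h5.k1
  rw [hcb0] at k1
  have hEn : (Codebook.entries v.mem c).toNat = E := by
    have h1 := sint32_cases E
    have h2 := k1.ent_nonneg
    have h3 := k1.ent_lt
    omega
  have ersi : (s_1143f3.reg .rsi).toNat % 2 ^ 32 = E := by
    rw [w_rsi_1143f3, hE, Vorbis.toNat_ofBV32, BitVec.toNat_ofNat]
    omega
  simp only [X86.User.Spec.footprint, vspec] at w_same
  have e_sp : (s_1143f3.reg .rsp).toNat + 8 = g.R := by
    rw [w_rsp_1143f3]
    unfold Ghost.R Ghost.RA steady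
    u_omega
  have e_a : (g.e.reg .rsp - 1488).toNat + 8 = g.R := by
    unfold Ghost.R Ghost.RA steady
    u_omega
  have e_rdi : (s_1143f3.reg .rdi).toNat = g.f := by
    rw [w_rdi_1143f3]
    exact hfN
  have hrsp' : s_1143f3r.reg .rsp = v.reg .rsp := by
    rw [w_rsp, hv_rsp]
  by_cases hfit : A.1.Fits ((s_1143f3.reg .rsi).toNat % 2 ^ 32)
  · -- the request fits: the ghost arena gets the temp block P1 = (lengths, E)
    obtain ⟨r1, r2, r3, r4, r5⟩ := temp_call_fits hfr hcur w_mem_1143f3 e_a e_sp e_rdi w_same w_post hfit w_rip hrsp'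
      (Vorbis.conv_code_eqOn w_code) w_inv (w_kept.get .r14 rfl)
    obtain ⟨h6, eent⟩ := In6.build h5 r1 r2 r3 r4 (w_kept.get .r12 rfl)
    refine ReachVia.done ⟨_, h6, Or.inr ?_⟩
    rw [r5, eent, hcb0, hEn, ersi]
    unfold TempsAre
    refine ⟨?_, ?_⟩
    · show (A.1.T - (r8 E + 32), E) :: A.1.temps = _
      rw [h5.noTemps]
      simp only [List.map_cons, List.map_nil]
      have eB : (A.1.pushTemp E).B = A.1.B := rfl
      have e1 : A.1.B + (A.1.T - (r8 E + 32)) - A.1.B = A.1.T - (r8 E + 32) := by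
        omega
      rw [eB, e1]
    · intro b hb
      rw [List.mem_singleton.mp hb]
      show A.1.B ≤ A.1.B + (A.1.T - (r8 E + 32))
      omega
  · -- the request does not fit: rax = 0, the same ghost
    obtain ⟨r1, r2, r3, r4, r5⟩ := temp_call_fail hfr hcur w_mem_1143f3 e_a e_sp e_rdi w_post hfit w_rip hrsp'
      (Vorbis.conv_code_eqOn w_code) w_inv (w_kept.get .r14 rfl)
    obtain ⟨h6, _⟩ := In6.build h5 r1 r2 r3 r4 (w_kept.get .r12 rfl)
    exact ReachVia.done ⟨A, h6, Or.inl r5⟩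

/-- `codeword_lengths` of the book under construction is still NULL after a step that writes nothing of the struct `cb(i)` (the sparse path:
the field is stored in segment C5 only). -/
theorem In6.step_cl {u₀ : State} {g : Ghost} {i : Nat} {A2 A3 Ai : Arena} {A' : Arena × List Obj} {pc : Word} {sp o : Nat}
    {v w : State} {ws : List Span} (h : In6 u₀ g i A2 A3 Ai A' pc sp o v) (hs : Mem.SameExcept ws v.mem w.mem)
    (hcb : g.cb w.mem i = g.cb v.mem i)
    (hoff : ∀ x, x ∈ ws → x.hi ≤ g.cb v.mem i ∨ g.cb v.mem i + 2120 ≤ x.lo) :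
    Codebook.codeword_lengths w.mem (g.cb w.mem i) = 0 := by
  have hcwh := (MInv.of h.frame h.cur).c_where
  have h0 := h.cl0
  rw [hcb]
  obtain ⟨c, hc⟩ : ∃ c, g.cb v.mem i = c := ⟨_, rfl⟩
  rw [hc] at hoff hcwh h0 ⊢
  have e1 : Mem.EqOn (c + 8) (c + 16) v.mem w.mem := by
    apply hs.eqOn
    intro x hx
    have := hoff x hx
    omega
  simp only [vacc, voff] at h0 ⊢
  rw [e1.u64 _ (by omega) (by omega) (by omega)]
  exact h0

/-- **Lines 3767 (second half) – 3773 on the sparse path** (`cut91` 0x1143f8: `rbx = rax ; test rbx, rbx ; je` ERRSTUB(3) → `AtERR` ;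
`test r12d, r12d ; jne` (not taken: a sparse book is not ordered) ; `ebp = 0 ; jmp` → `AtC4` with the temp block P1). -/
theorem sparse2 {Lay : Layout} (hLay : Lay.hi = 0x1000000) {μ : Microarch} (hμ : UserX.MicroOK μ) {u₀ : State}
    (hcode : HasCodeNat Lay u₀ Vorbis.L.start_decoder.entry Vorbis.Code.code_start_decoder.nat Vorbis.L.start_decoder.size)
    (h_error : ∀ (others : List Obj) (frames : List (Nat × FrameLayout)),
      Calls Lay μ Vorbis.WayInv (Vorbis.conv u₀) Vorbis.L.error.entry (Vorbis.Spec.error.spec others frames))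
    (g : Ghost) (i : Nat) (v : State) (A2 A3 Ai : Arena) (A : Arena × List Obj) (o : Nat)
    (h6 : In6 u₀ g i A2 A3 Ai A Vorbis.L.start_decoder.cut91 1 o v)
    (hal : v.reg .rax = 0 ∨ TempsAre A.1 [((v.reg .rax).toNat, (Codebook.entries v.mem (g.cb v.mem i)).toNat)]) :
    ReachVia Lay μ WayInv v (fun w => AtC3 u₀ g i w ∨ AtC4 u₀ g i w ∨ AtC16 u₀ g w ∨ AtERR u₀ g w) := by
  have hfr := h6.frame
  have hcur := h6.cur
  have hh := hcur.hand
  have he := hfr.entry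
  v_entry he
  simp only [depth] at he_room he_stack
  have hpos : Pos g A := Pos.of hfr hcur
  have hwhere := f_where hfr hh
  have hRA : g.RA = (g.e.reg .rsp).toNat := rfl
  rw [hRA] at hwhere
  have w_rip : v.rip = Vorbis.L.start_decoder.cut91 := hfr.rip
  have hv_rsp : v.reg .rsp = g.e.reg .rsp - 1480 := by
    rw [hfr.rsp]
    unfold Ghost.R Ghost.RA steady
    have := slot_word (g.e.reg .rsp) 0 (by omega) (by omega)
    simpa using this
  obtain ⟨c, hcb0⟩ : ∃ c, g.cb v.mem i = c := ⟨_, rfl⟩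
  have w_eq : Mem.EqOn Vorbis.L.textLo Vorbis.L.textHi u₀.mem v.mem := hfr.code
  have hdf : v.flags .df = false := (show abiInv _ from hfr.inv).1
  have hmx : v.mxcsr &&& 0x1F80 = 0x1F80 := (show abiInv _ from hfr.inv).2
  have hsse := Vorbis.sseOK_of_abiInv hfr.inv
  have hfN : (UInt64.ofNat g.f).toNat = g.f := by u_omega
  have hcwh := (MInv.of hfr hcur).c_where
  have htext := hh.arenaText
  have htx : Vorbis.L.textHi = 0x119d40 := rfl
  have hout := hpos.objOut
  rw [hcb0] at hcwh
  rw [htx] at htext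
  have hcw : 0x119d40 ≤ c ∧ c + 2120 ≤ 0xC00000 ∧ (c + 2120 ≤ 0x700000 ∨ 0x800000 ≤ c) ∧
      (g.f + 1808 ≤ c ∨ c + 2120 ≤ g.f) := by
    omega
  have hcar : A.1.B ≤ c ∧ c + 2120 ≤ A.1.B + A.1.L := hcwh.1
  clear hcwh htext hout
  have hv_r12 : v.reg .r12 = UInt64.ofNat o := h6.r12
  have hv_f : v.mem.readLE (g.e.reg .rsp - 1456) 8 = g.f := by
    have := hcur.slot_f
    unfold Mem.u64 Ghost.R Ghost.RA steady at this
    rw [slot_word (g.e.reg .rsp) 0x18 (by omega) (by omega)] at this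
    exact this
  have herr := h_error A.2 g.frames'
  have hl : LiveIn A.2 g.frames' g.f 1808 := hh.obj.mono (sub_frames' g A)
  obtain ⟨p, hp⟩ : ∃ p, (v.reg .rax).toNat = p := ⟨_, rfl⟩
  have hv_rax : v.reg .rax = UInt64.ofNat p := by
    rw [← hp]
    exact (UInt64.ofNat_toNat).symm
  have hpN : (UInt64.ofNat p).toNat = p := by
    rw [← hv_rax]
    exact hp
  have hreq := hpos.r_eq
  rw [hRA] at hreq
  u_walk hcode [hμ.vendor] until [Vorbis.L.start_decoder.cut4, Vorbis.L.start_decoder.cut101, Vorbis.L.start_decoder.cut122] span [Vorbis.L.textLo, Vorbis.L.textHi] side (v_side)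
  case call_inv => v_inv
  case pre_1144e4 =>
    -- the precondition of error(f, VORBIS_outofmem) at 0x1144e4
    have hun : ShadowUntouched v.mem s_1144e4.mem := by v_untouched
    have hrdi : (s_1144e4.reg .rdi).toNat = g.f := by
      rw [w_rdi]
      exact hfN
    refine ⟨shadowPre_call hfr ?_ hun, ?_⟩
    · rw [w_rsp]
      unfold Ghost.R Ghost.RA steady
      u_omega
    · rw [hrdi]
      exact hl
  · -- after error returned (0x1144e9 `jmp 113b22`): the exit AtERR with eax = 0 (line 3771, `lengths = NULL`)
    obtain ⟨hrax, hunp, _⟩ := w_post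
    v_after_call w_rsp_1144e4 w_mem_1144e4
    simp only [w_rdi_1144e4, hfN, voff] at w_same
    have hs0 : Mem.SameExcept [⟨(g.e.reg .rsp).toNat - 1888, (g.e.reg .rsp).toNat - 1480⟩,
        ⟨g.f + 140, g.f + 144⟩] v.mem s_1144e4r.mem := by
      u_same
    have hun0 : ShadowUntouched v.mem s_1144e4r.mem := by v_untouched
    have w_rax : s_1144e4r.reg .rax = 0 := hrax
    u_walk hcode [hμ.vendor] until [Vorbis.L.start_decoder.cut4] span [Vorbis.L.textLo, Vorbis.L.textHi] side (v_side)
    have hs : Mem.SameExcept [⟨(g.e.reg .rsp).toNat - 1888, (g.e.reg .rsp).toNat - 1480⟩,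
        ⟨g.f + 140, g.f + 144⟩] v.mem s_1144e9.mem := by
      rw [w_mem]
      exact hs0
    have hun : ShadowUntouched v.mem s_1144e9.mem := by
      rw [w_mem]
      exact hun0
    have hrsp : s_1144e9.reg .rsp = v.reg .rsp := by
      rw [w_rsp, hv_rsp]
    have hinv : abiInv s_1144e9 := by v_inv
    have hb : Bits (g.Blk A) g.len s_1144e9.mem g.f := by
      apply bits_kept hpos hcur.sd.bits hs
      intro x hx
      simp only [List.mem_cons, List.mem_nil_iff, or_false] at hx
      rcases hx with rfl | rfl <;> simp only [] <;> omega
    have hout := In6.step (pc' := pc_ERR) h6 hs hun (by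
      intro x hx
      rw [hcb0]
      simp only [List.mem_cons, List.mem_nil_iff, or_false] at hx
      unfold OkWin0
      rcases hx with rfl | rfl <;> simp only [] <;> omega) (by
      intro x hx
      rw [hcb0]
      simp only [List.mem_cons, List.mem_nil_iff, or_false] at hx
      rcases hx with rfl | rfl <;> simp only [] <;> omega) hb w_rip hrsp w_eq hinv (w_kept .r14 rfl) (w_kept .r12 rfl)
    refine ReachVia.done (Or.inr (Or.inr (Or.inr (exitERR hout ?_))))
    rw [w_rax]
    rfl
  · -- 0x1144ee (`cut101`) is not reached: `ordered ≠ 0` gives sparse = 0 (Z10), but this is the sparse path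
    exfalso
    have ho := h6.o_lt
    have e32 : (Word.part Width.w32 (UInt64.ofNat o)).toNat = o := by
      rw [Vorbis.toNat_part32]
      have : (UInt64.ofNat o).toNat = o := by u_omega
      omega
    have hone := h6.ord (by omega)
    exact absurd hone (by decide)
  · -- 0x1147c3 (`cut122`), `ordered = 0`: the exit AtC4 with j = total = 0, the temp block P1
    have hs : Mem.SameExcept [] v.mem s_114410.mem := by
      rw [w_mem]
      exact Mem.SameExcept.refl _ _
    have hun : ShadowUntouched v.mem s_114410.mem := by
      rw [w_mem]
      exact Mem.EqOn.refl _ _ _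
    have hinv : abiInv s_114410 := by v_inv
    have hb : Bits (g.Blk A) g.len s_114410.mem g.f := by
      rw [w_mem]
      exact hcur.sd.bits
    have hout := In6.step (pc' := pc_C4) h6 hs hun (fun x hx => absurd hx List.not_mem_nil)
      (fun x hx => absurd hx List.not_mem_nil) hb w_rip (w_kept .rsp rfl) w_eq hinv (w_kept .r14 rfl) (w_kept .r12 rfl)
    have hcl := In6.step_cl h6 hs hout.cb (fun x hx => absurd hx List.not_mem_nil)
    have hpne : v.reg .rax ≠ 0 := by
      intro h0
      rw [hv_rax] at h0
      apply hbr_1143fe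
      rw [h0]
      rfl
    have htemps := hal.resolve_left hpne
    rw [hp] at htemps
    have ho0 : o = 0 := by
      have ho := h6.o_lt
      have e32 : (Word.part Width.w32 (UInt64.ofNat o)).toNat = o := by
        rw [Vorbis.toNat_part32]
        have : (UInt64.ofNat o).toNat = o := by u_omega
        omega
      omega
    subst ho0
    refine ReachVia.done (Or.inr (Or.inl (exitC4 (p := p) hout ?_ ?_ ?_)))
    · rw [w_rbx]
      rfl
    · rw [w_rbp]
      rfl
    · exact
        { sparse_01 := Or.inr hout.sparse
          sparse_temp := fun _ => by rw [hout.entries]; exact htemps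
          sparse_null := fun _ => hcl
          dense_block := fun h0 => absurd (hout.sparse.symm.trans h0) (by decide)
          dense_eq := fun h0 => absurd (hout.sparse.symm.trans h0) (by decide)
          dense_temps := fun h0 => absurd (hout.sparse.symm.trans h0) (by decide) }

/-- **SEGMENT C2, COMPOSED** (0x114298 … the exits 0x1151bf `AtC16`, 0x1144ee `AtC3`, 0x1147c3 `AtC4`, 0x113b22 `AtERR`): `to_cut90` (the head, the
sync pattern, `dimensions`, `entries`, `ordered`), `ord1` / `ord2` (the dispatch on `ordered`, `sparse`), `fix6b` (the store of `sparse`, FIX 6),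
then the sparse (`sparse1`, `sparse2`: setup_temp_malloc) or the dense (`dense1`, `dense2`: setup_malloc) allocation of `lengths`. -/
theorem seg_c2 {Lay : Layout} (hLay : Lay.hi = 0x1000000) {μ : Microarch} (hμ : UserX.MicroOK μ) {u₀ : State}
    (hcode : HasCodeNat Lay u₀ Vorbis.L.start_decoder.entry Vorbis.Code.code_start_decoder.nat Vorbis.L.start_decoder.size)
    (hld4 : Asan.SmallCheck Lay μ Vorbis.WayInv (Vorbis.CodeOK u₀) [.rax, .rcx, .rdx] 4 Vorbis.L.__asan_load4_noabort.entry)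
    (hld8 : Asan.SmallCheck Lay μ Vorbis.WayInv (Vorbis.CodeOK u₀) [.rax, .rcx, .rdx] 8 Vorbis.L.__asan_load8_noabort.entry)
    (h_get_bits : ∀ (others : List Obj) (frames : List (Nat × FrameLayout)) (Blk : Block → Prop) (len : Nat),
      Calls Lay μ Vorbis.WayInv (Vorbis.conv u₀) Vorbis.L.get_bits.entry (Vorbis.Spec.get_bits.spec others frames Blk len))
    (hst4 : Asan.SmallCheck Lay μ Vorbis.WayInv (Vorbis.CodeOK u₀) [.rax, .rcx, .rdx] 4 Vorbis.L.__asan_store4_noabort.entry)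
    (hst1 : Asan.SmallCheck Lay μ Vorbis.WayInv (Vorbis.CodeOK u₀) [.rax, .rdx] 1 Vorbis.L.__asan_store1_noabort.entry)
    (h_tmalloc : ∀ (others : List Obj) (frames : List (Nat × FrameLayout)) (A : Arena),
      Calls Lay μ Vorbis.WayInv (Vorbis.conv u₀) Vorbis.L.setup_temp_malloc.entry (Vorbis.Spec.setup_temp_malloc.spec others frames A))
    (h_error : ∀ (others : List Obj) (frames : List (Nat × FrameLayout)),
      Calls Lay μ Vorbis.WayInv (Vorbis.conv u₀) Vorbis.L.error.entry (Vorbis.Spec.error.spec others frames))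
    (h_malloc : ∀ (others : List Obj) (frames : List (Nat × FrameLayout)) (A : Arena),
      Calls Lay μ Vorbis.WayInv (Vorbis.conv u₀) Vorbis.L.setup_malloc.entry (Vorbis.Spec.setup_malloc.spec others frames A))
    (hst8 : Asan.SmallCheck Lay μ Vorbis.WayInv (Vorbis.CodeOK u₀) [.rax, .rcx, .rdx] 8 Vorbis.L.__asan_store8_noabort.entry) :
    SegC2 Lay μ u₀ := by
  intro g i v hat
  -- lines 3746 – 3761: the head of the loop … `ordered = get_bits(f, 1)` (`cut90`)
  refine (to_cut90 hLay hμ hcode hld4 hld8 h_get_bits hst4 h_error g i v hat).trans ?_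
  intro v1 h1
  rcases h1 with h16 | herr | ⟨A, A2, A3, h1⟩
  · exact ReachVia.done (Or.inr (Or.inr (Or.inl h16)))
  · exact ReachVia.done (Or.inr (Or.inr (Or.inr herr)))
  -- line 3762: the dispatch on `ordered`, the join at `chk41`
  have hjoin : ReachVia Lay μ WayInv v1 (fun w => In4 u₀ g i A2 A3 A Vorbis.L.start_decoder.chk41 w) := by
    refine (ord1 hLay hμ hcode h_get_bits g i v1 A2 A3 A h1).trans ?_
    intro v2 h2
    rcases h2 with h4 | hz
    · exact ReachVia.done h4
    · exact ord2 hLay hμ hcode h_get_bits g i v2 A2 A3 A hz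
  refine hjoin.trans ?_
  intro v3 h3
  -- lines 3762 – 3769: `c->sparse`, FIX 6, the check of `c->entries` before the allocator call
  refine (fix6b hLay hμ hcode hst1 hld4 h_error h_get_bits g i v3 A2 A3 A h3).trans ?_
  intro v4 h4
  rcases h4 with herr | ⟨o, h5⟩ | ⟨o, h5⟩
  · exact ReachVia.done (Or.inr (Or.inr (Or.inr herr)))
  · -- the sparse path: setup_temp_malloc, lines 3767, 3771, 3773
    refine (sparse1 hLay hμ hcode h_tmalloc g i v4 A2 A3 A o h5).trans ?_
    intro v5 h5r
    obtain ⟨A', h6, hal⟩ := h5r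
    exact sparse2 hLay hμ hcode h_error g i v5 A2 A3 A.1 A' o h6 hal
  · -- the dense path: setup_malloc, lines 3769, 3771, 3773
    refine (dense1 hLay hμ hcode h_malloc g i v4 A2 A3 A o h5).trans ?_
    intro v5 h5r
    obtain ⟨A', h6, hnt, hal⟩ := h5r
    exact dense2 hLay hμ hcode hst8 h_error g i v5 A2 A3 A.1 A' o h6 hnt hal

end Vorbis.Spec.start_decoder_C2
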